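/-
  THE TEST MATRIX OF THE STEPPER (generated: tools/steptest/gen.py final; the byte strings are GNU as's, or the image's own).
  One `example` per instruction form: `u_insn` runs the decoded term (`insn% [bytes]`: found by the model's decoder)
  from a state whose sixteen registers, RIP and RFLAGS are named, and leaves
      side_has         L.Has a n             one per memory access, in program order (closed here by `hHas`)
      side_canonical   target < 40000000H    an indirect branch target, a return address (`hCan`)
      side_nofault     False                 under `hopt1 : Alu.div … = none`: DIV / IDIV must not raise #DE (`hNF`)
      side_req         a `require` that does not evaluate (multi-byte NOP: the processor's family, `hfam`)
      cont             Q u'                  (`hQ`)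
  The hypotheses `hHas` … are there to CLOSE goals of exactly these shapes (they are not meant to be satisfiable): the
  test is that the tactic gets through and leaves nothing else. The shapes themselves are in STEP-RESULTS.txt.
  The forms that do NOT get through are at the end (`u_expect_blocked`), each with the reason.
-/
import UserX.InsnTerm
open X86 X86.Sem X86.User

set_option linter.unusedSimpArgs false
set_option linter.unusedVariables false
set_option maxRecDepth 2000

section
variable (L : Layout) (μ : Microarch) (u : State) (Q : State → Prop)
variable (rax rcx rdx rbx rsp rbp rsi rdi r8 r9 r10 r11 r12 r13 r14 r15 : Word) (fl : Flags)

/-- `mov rdi, rbx` -/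
example (h_rax : u.reg .rax = rax) (h_rcx : u.reg .rcx = rcx) (h_rdx : u.reg .rdx = rdx) (h_rbx : u.reg .rbx = rbx) (h_rsp : u.reg .rsp = rsp) (h_rbp : u.reg .rbp = rbp) (h_rsi : u.reg .rsi = rsi) (h_rdi : u.reg .rdi = rdi) (h_r8 : u.reg .r8 = r8) (h_r9 : u.reg .r9 = r9) (h_r10 : u.reg .r10 = r10) (h_r11 : u.reg .r11 = r11) (h_r12 : u.reg .r12 = r12) (h_r13 : u.reg .r13 = r13) (h_r14 : u.reg .r14 = r14) (h_r15 : u.reg .r15 = r15) (h_rip : u.rip = 0x100000) (h_fl : u.flags = fl) (hμ : μ.vendor = .intel)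
    (hHas : ∀ a n, L.Has a n) (hCan : ∀ a : Word, a < 0x40000000)
    (hNF : ∀ {α : Type} (x : Option α), x ≠ none) (hfam : μ.cfg.field Feature.familyId = 6) (hQ : ∀ v, Q v) :
    InsnGoal L μ u Q (insn% [0x48, 0x89, 0xdf]) := by
  u_insn [h_rax, h_rcx, h_rdx, h_rbx, h_rsp, h_rbp, h_rsi, h_rdi, h_r8, h_r9, h_r10, h_r11, h_r12, h_r13, h_r14, h_r15, h_rip, h_fl, hμ]
  all_goals first | exact hHas _ _ | exact hCan _ | exact hNF _ hopt1 | exact Or.inl hfam | exact hQ _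

/-- `mov ebp, eax` -/
example (h_rax : u.reg .rax = rax) (h_rcx : u.reg .rcx = rcx) (h_rdx : u.reg .rdx = rdx) (h_rbx : u.reg .rbx = rbx) (h_rsp : u.reg .rsp = rsp) (h_rbp : u.reg .rbp = rbp) (h_rsi : u.reg .rsi = rsi) (h_rdi : u.reg .rdi = rdi) (h_r8 : u.reg .r8 = r8) (h_r9 : u.reg .r9 = r9) (h_r10 : u.reg .r10 = r10) (h_r11 : u.reg .r11 = r11) (h_r12 : u.reg .r12 = r12) (h_r13 : u.reg .r13 = r13) (h_r14 : u.reg .r14 = r14) (h_r15 : u.reg .r15 = r15) (h_rip : u.rip = 0x100000) (h_fl : u.flags = fl) (hμ : μ.vendor = .intel)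
    (hHas : ∀ a n, L.Has a n) (hCan : ∀ a : Word, a < 0x40000000)
    (hNF : ∀ {α : Type} (x : Option α), x ≠ none) (hfam : μ.cfg.field Feature.familyId = 6) (hQ : ∀ v, Q v) :
    InsnGoal L μ u Q (insn% [0x89, 0xc5]) := by
  u_insn [h_rax, h_rcx, h_rdx, h_rbx, h_rsp, h_rbp, h_rsi, h_rdi, h_r8, h_r9, h_r10, h_r11, h_r12, h_r13, h_r14, h_r15, h_rip, h_fl, hμ]
  all_goals first | exact hHas _ _ | exact hCan _ | exact hNF _ hopt1 | exact Or.inl hfam | exact hQ _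

/-- `mov cx, dx` -/
example (h_rax : u.reg .rax = rax) (h_rcx : u.reg .rcx = rcx) (h_rdx : u.reg .rdx = rdx) (h_rbx : u.reg .rbx = rbx) (h_rsp : u.reg .rsp = rsp) (h_rbp : u.reg .rbp = rbp) (h_rsi : u.reg .rsi = rsi) (h_rdi : u.reg .rdi = rdi) (h_r8 : u.reg .r8 = r8) (h_r9 : u.reg .r9 = r9) (h_r10 : u.reg .r10 = r10) (h_r11 : u.reg .r11 = r11) (h_r12 : u.reg .r12 = r12) (h_r13 : u.reg .r13 = r13) (h_r14 : u.reg .r14 = r14) (h_r15 : u.reg .r15 = r15) (h_rip : u.rip = 0x100000) (h_fl : u.flags = fl) (hμ : μ.vendor = .intel)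
    (hHas : ∀ a n, L.Has a n) (hCan : ∀ a : Word, a < 0x40000000)
    (hNF : ∀ {α : Type} (x : Option α), x ≠ none) (hfam : μ.cfg.field Feature.familyId = 6) (hQ : ∀ v, Q v) :
    InsnGoal L μ u Q (insn% [0x66, 0x89, 0xd1]) := by
  u_insn [h_rax, h_rcx, h_rdx, h_rbx, h_rsp, h_rbp, h_rsi, h_rdi, h_r8, h_r9, h_r10, h_r11, h_r12, h_r13, h_r14, h_r15, h_rip, h_fl, hμ]
  all_goals first | exact hHas _ _ | exact hCan _ | exact hNF _ hopt1 | exact Or.inl hfam | exact hQ _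

/-- `mov cl, dl` -/
example (h_rax : u.reg .rax = rax) (h_rcx : u.reg .rcx = rcx) (h_rdx : u.reg .rdx = rdx) (h_rbx : u.reg .rbx = rbx) (h_rsp : u.reg .rsp = rsp) (h_rbp : u.reg .rbp = rbp) (h_rsi : u.reg .rsi = rsi) (h_rdi : u.reg .rdi = rdi) (h_r8 : u.reg .r8 = r8) (h_r9 : u.reg .r9 = r9) (h_r10 : u.reg .r10 = r10) (h_r11 : u.reg .r11 = r11) (h_r12 : u.reg .r12 = r12) (h_r13 : u.reg .r13 = r13) (h_r14 : u.reg .r14 = r14) (h_r15 : u.reg .r15 = r15) (h_rip : u.rip = 0x100000) (h_fl : u.flags = fl) (hμ : μ.vendor = .intel)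
    (hHas : ∀ a n, L.Has a n) (hCan : ∀ a : Word, a < 0x40000000)
    (hNF : ∀ {α : Type} (x : Option α), x ≠ none) (hfam : μ.cfg.field Feature.familyId = 6) (hQ : ∀ v, Q v) :
    InsnGoal L μ u Q (insn% [0x88, 0xd1]) := by
  u_insn [h_rax, h_rcx, h_rdx, h_rbx, h_rsp, h_rbp, h_rsi, h_rdi, h_r8, h_r9, h_r10, h_r11, h_r12, h_r13, h_r14, h_r15, h_rip, h_fl, hμ]
  all_goals first | exact hHas _ _ | exact hCan _ | exact hNF _ hopt1 | exact Or.inl hfam | exact hQ _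

/-- `mov cl, ah` -/
example (h_rax : u.reg .rax = rax) (h_rcx : u.reg .rcx = rcx) (h_rdx : u.reg .rdx = rdx) (h_rbx : u.reg .rbx = rbx) (h_rsp : u.reg .rsp = rsp) (h_rbp : u.reg .rbp = rbp) (h_rsi : u.reg .rsi = rsi) (h_rdi : u.reg .rdi = rdi) (h_r8 : u.reg .r8 = r8) (h_r9 : u.reg .r9 = r9) (h_r10 : u.reg .r10 = r10) (h_r11 : u.reg .r11 = r11) (h_r12 : u.reg .r12 = r12) (h_r13 : u.reg .r13 = r13) (h_r14 : u.reg .r14 = r14) (h_r15 : u.reg .r15 = r15) (h_rip : u.rip = 0x100000) (h_fl : u.flags = fl) (hμ : μ.vendor = .intel)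
    (hHas : ∀ a n, L.Has a n) (hCan : ∀ a : Word, a < 0x40000000)
    (hNF : ∀ {α : Type} (x : Option α), x ≠ none) (hfam : μ.cfg.field Feature.familyId = 6) (hQ : ∀ v, Q v) :
    InsnGoal L μ u Q (insn% [0x88, 0xe1]) := by
  u_insn [h_rax, h_rcx, h_rdx, h_rbx, h_rsp, h_rbp, h_rsi, h_rdi, h_r8, h_r9, h_r10, h_r11, h_r12, h_r13, h_r14, h_r15, h_rip, h_fl, hμ]
  all_goals first | exact hHas _ _ | exact hCan _ | exact hNF _ hopt1 | exact Or.inl hfam | exact hQ _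

/-- `mov esi, 0x14` -/
example (h_rax : u.reg .rax = rax) (h_rcx : u.reg .rcx = rcx) (h_rdx : u.reg .rdx = rdx) (h_rbx : u.reg .rbx = rbx) (h_rsp : u.reg .rsp = rsp) (h_rbp : u.reg .rbp = rbp) (h_rsi : u.reg .rsi = rsi) (h_rdi : u.reg .rdi = rdi) (h_r8 : u.reg .r8 = r8) (h_r9 : u.reg .r9 = r9) (h_r10 : u.reg .r10 = r10) (h_r11 : u.reg .r11 = r11) (h_r12 : u.reg .r12 = r12) (h_r13 : u.reg .r13 = r13) (h_r14 : u.reg .r14 = r14) (h_r15 : u.reg .r15 = r15) (h_rip : u.rip = 0x100000) (h_fl : u.flags = fl) (hμ : μ.vendor = .intel)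
    (hHas : ∀ a n, L.Has a n) (hCan : ∀ a : Word, a < 0x40000000)
    (hNF : ∀ {α : Type} (x : Option α), x ≠ none) (hfam : μ.cfg.field Feature.familyId = 6) (hQ : ∀ v, Q v) :
    InsnGoal L μ u Q (insn% [0xbe, 0x14, 0x00, 0x00, 0x00]) := by
  u_insn [h_rax, h_rcx, h_rdx, h_rbx, h_rsp, h_rbp, h_rsi, h_rdi, h_r8, h_r9, h_r10, h_r11, h_r12, h_r13, h_r14, h_r15, h_rip, h_fl, hμ]
  all_goals first | exact hHas _ _ | exact hCan _ | exact hNF _ hopt1 | exact Or.inl hfam | exact hQ _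

/-- `mov rax, -1` -/
example (h_rax : u.reg .rax = rax) (h_rcx : u.reg .rcx = rcx) (h_rdx : u.reg .rdx = rdx) (h_rbx : u.reg .rbx = rbx) (h_rsp : u.reg .rsp = rsp) (h_rbp : u.reg .rbp = rbp) (h_rsi : u.reg .rsi = rsi) (h_rdi : u.reg .rdi = rdi) (h_r8 : u.reg .r8 = r8) (h_r9 : u.reg .r9 = r9) (h_r10 : u.reg .r10 = r10) (h_r11 : u.reg .r11 = r11) (h_r12 : u.reg .r12 = r12) (h_r13 : u.reg .r13 = r13) (h_r14 : u.reg .r14 = r14) (h_r15 : u.reg .r15 = r15) (h_rip : u.rip = 0x100000) (h_fl : u.flags = fl) (hμ : μ.vendor = .intel)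
    (hHas : ∀ a n, L.Has a n) (hCan : ∀ a : Word, a < 0x40000000)
    (hNF : ∀ {α : Type} (x : Option α), x ≠ none) (hfam : μ.cfg.field Feature.familyId = 6) (hQ : ∀ v, Q v) :
    InsnGoal L μ u Q (insn% [0x48, 0xc7, 0xc0, 0xff, 0xff, 0xff, 0xff]) := by
  u_insn [h_rax, h_rcx, h_rdx, h_rbx, h_rsp, h_rbp, h_rsi, h_rdi, h_r8, h_r9, h_r10, h_r11, h_r12, h_r13, h_r14, h_r15, h_rip, h_fl, hμ]
  all_goals first | exact hHas _ _ | exact hCan _ | exact hNF _ hopt1 | exact Or.inl hfam | exact hQ _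

/-- `movabs rsi, 0xfffffffffffff` -/
example (h_rax : u.reg .rax = rax) (h_rcx : u.reg .rcx = rcx) (h_rdx : u.reg .rdx = rdx) (h_rbx : u.reg .rbx = rbx) (h_rsp : u.reg .rsp = rsp) (h_rbp : u.reg .rbp = rbp) (h_rsi : u.reg .rsi = rsi) (h_rdi : u.reg .rdi = rdi) (h_r8 : u.reg .r8 = r8) (h_r9 : u.reg .r9 = r9) (h_r10 : u.reg .r10 = r10) (h_r11 : u.reg .r11 = r11) (h_r12 : u.reg .r12 = r12) (h_r13 : u.reg .r13 = r13) (h_r14 : u.reg .r14 = r14) (h_r15 : u.reg .r15 = r15) (h_rip : u.rip = 0x100000) (h_fl : u.flags = fl) (hμ : μ.vendor = .intel)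
    (hHas : ∀ a n, L.Has a n) (hCan : ∀ a : Word, a < 0x40000000)
    (hNF : ∀ {α : Type} (x : Option α), x ≠ none) (hfam : μ.cfg.field Feature.familyId = 6) (hQ : ∀ v, Q v) :
    InsnGoal L μ u Q (insn% [0x48, 0xbe, 0xff, 0xff, 0xff, 0xff, 0xff, 0xff, 0x0f, 0x00]) := by
  u_insn [h_rax, h_rcx, h_rdx, h_rbx, h_rsp, h_rbp, h_rsi, h_rdi, h_r8, h_r9, h_r10, h_r11, h_r12, h_r13, h_r14, h_r15, h_rip, h_fl, hμ]
  all_goals first | exact hHas _ _ | exact hCan _ | exact hNF _ hopt1 | exact Or.inl hfam | exact hQ _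

/-- `mov ax, 0x1234` -/
example (h_rax : u.reg .rax = rax) (h_rcx : u.reg .rcx = rcx) (h_rdx : u.reg .rdx = rdx) (h_rbx : u.reg .rbx = rbx) (h_rsp : u.reg .rsp = rsp) (h_rbp : u.reg .rbp = rbp) (h_rsi : u.reg .rsi = rsi) (h_rdi : u.reg .rdi = rdi) (h_r8 : u.reg .r8 = r8) (h_r9 : u.reg .r9 = r9) (h_r10 : u.reg .r10 = r10) (h_r11 : u.reg .r11 = r11) (h_r12 : u.reg .r12 = r12) (h_r13 : u.reg .r13 = r13) (h_r14 : u.reg .r14 = r14) (h_r15 : u.reg .r15 = r15) (h_rip : u.rip = 0x100000) (h_fl : u.flags = fl) (hμ : μ.vendor = .intel)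
    (hHas : ∀ a n, L.Has a n) (hCan : ∀ a : Word, a < 0x40000000)
    (hNF : ∀ {α : Type} (x : Option α), x ≠ none) (hfam : μ.cfg.field Feature.familyId = 6) (hQ : ∀ v, Q v) :
    InsnGoal L μ u Q (insn% [0x66, 0xb8, 0x34, 0x12]) := by
  u_insn [h_rax, h_rcx, h_rdx, h_rbx, h_rsp, h_rbp, h_rsi, h_rdi, h_r8, h_r9, h_r10, h_r11, h_r12, h_r13, h_r14, h_r15, h_rip, h_fl, hμ]
  all_goals first | exact hHas _ _ | exact hCan _ | exact hNF _ hopt1 | exact Or.inl hfam | exact hQ _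

/-- `mov al, 0x7f` -/
example (h_rax : u.reg .rax = rax) (h_rcx : u.reg .rcx = rcx) (h_rdx : u.reg .rdx = rdx) (h_rbx : u.reg .rbx = rbx) (h_rsp : u.reg .rsp = rsp) (h_rbp : u.reg .rbp = rbp) (h_rsi : u.reg .rsi = rsi) (h_rdi : u.reg .rdi = rdi) (h_r8 : u.reg .r8 = r8) (h_r9 : u.reg .r9 = r9) (h_r10 : u.reg .r10 = r10) (h_r11 : u.reg .r11 = r11) (h_r12 : u.reg .r12 = r12) (h_r13 : u.reg .r13 = r13) (h_r14 : u.reg .r14 = r14) (h_r15 : u.reg .r15 = r15) (h_rip : u.rip = 0x100000) (h_fl : u.flags = fl) (hμ : μ.vendor = .intel)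
    (hHas : ∀ a n, L.Has a n) (hCan : ∀ a : Word, a < 0x40000000)
    (hNF : ∀ {α : Type} (x : Option α), x ≠ none) (hfam : μ.cfg.field Feature.familyId = 6) (hQ : ∀ v, Q v) :
    InsnGoal L μ u Q (insn% [0xb0, 0x7f]) := by
  u_insn [h_rax, h_rcx, h_rdx, h_rbx, h_rsp, h_rbp, h_rsi, h_rdi, h_r8, h_r9, h_r10, h_r11, h_r12, h_r13, h_r14, h_r15, h_rip, h_fl, hμ]
  all_goals first | exact hHas _ _ | exact hCan _ | exact hNF _ hopt1 | exact Or.inl hfam | exact hQ _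

/-- `mov rdi, qword ptr [rsp+0x8]` -/
example (h_rax : u.reg .rax = rax) (h_rcx : u.reg .rcx = rcx) (h_rdx : u.reg .rdx = rdx) (h_rbx : u.reg .rbx = rbx) (h_rsp : u.reg .rsp = rsp) (h_rbp : u.reg .rbp = rbp) (h_rsi : u.reg .rsi = rsi) (h_rdi : u.reg .rdi = rdi) (h_r8 : u.reg .r8 = r8) (h_r9 : u.reg .r9 = r9) (h_r10 : u.reg .r10 = r10) (h_r11 : u.reg .r11 = r11) (h_r12 : u.reg .r12 = r12) (h_r13 : u.reg .r13 = r13) (h_r14 : u.reg .r14 = r14) (h_r15 : u.reg .r15 = r15) (h_rip : u.rip = 0x100000) (h_fl : u.flags = fl) (hμ : μ.vendor = .intel)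
    (hHas : ∀ a n, L.Has a n) (hCan : ∀ a : Word, a < 0x40000000)
    (hNF : ∀ {α : Type} (x : Option α), x ≠ none) (hfam : μ.cfg.field Feature.familyId = 6) (hQ : ∀ v, Q v) :
    InsnGoal L μ u Q (insn% [0x48, 0x8b, 0x7c, 0x24, 0x08]) := by
  u_insn [h_rax, h_rcx, h_rdx, h_rbx, h_rsp, h_rbp, h_rsi, h_rdi, h_r8, h_r9, h_r10, h_r11, h_r12, h_r13, h_r14, h_r15, h_rip, h_fl, hμ]
  all_goals first | exact hHas _ _ | exact hCan _ | exact hNF _ hopt1 | exact Or.inl hfam | exact hQ _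

/-- `mov eax, dword ptr [r14+0x840]` -/
example (h_rax : u.reg .rax = rax) (h_rcx : u.reg .rcx = rcx) (h_rdx : u.reg .rdx = rdx) (h_rbx : u.reg .rbx = rbx) (h_rsp : u.reg .rsp = rsp) (h_rbp : u.reg .rbp = rbp) (h_rsi : u.reg .rsi = rsi) (h_rdi : u.reg .rdi = rdi) (h_r8 : u.reg .r8 = r8) (h_r9 : u.reg .r9 = r9) (h_r10 : u.reg .r10 = r10) (h_r11 : u.reg .r11 = r11) (h_r12 : u.reg .r12 = r12) (h_r13 : u.reg .r13 = r13) (h_r14 : u.reg .r14 = r14) (h_r15 : u.reg .r15 = r15) (h_rip : u.rip = 0x100000) (h_fl : u.flags = fl) (hμ : μ.vendor = .intel)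
    (hHas : ∀ a n, L.Has a n) (hCan : ∀ a : Word, a < 0x40000000)
    (hNF : ∀ {α : Type} (x : Option α), x ≠ none) (hfam : μ.cfg.field Feature.familyId = 6) (hQ : ∀ v, Q v) :
    InsnGoal L μ u Q (insn% [0x41, 0x8b, 0x86, 0x40, 0x08, 0x00, 0x00]) := by
  u_insn [h_rax, h_rcx, h_rdx, h_rbx, h_rsp, h_rbp, h_rsi, h_rdi, h_r8, h_r9, h_r10, h_r11, h_r12, h_r13, h_r14, h_r15, h_rip, h_fl, hμ]
  all_goals first | exact hHas _ _ | exact hCan _ | exact hNF _ hopt1 | exact Or.inl hfam | exact hQ _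

/-- `mov ax, word ptr [rbx+2]` -/
example (h_rax : u.reg .rax = rax) (h_rcx : u.reg .rcx = rcx) (h_rdx : u.reg .rdx = rdx) (h_rbx : u.reg .rbx = rbx) (h_rsp : u.reg .rsp = rsp) (h_rbp : u.reg .rbp = rbp) (h_rsi : u.reg .rsi = rsi) (h_rdi : u.reg .rdi = rdi) (h_r8 : u.reg .r8 = r8) (h_r9 : u.reg .r9 = r9) (h_r10 : u.reg .r10 = r10) (h_r11 : u.reg .r11 = r11) (h_r12 : u.reg .r12 = r12) (h_r13 : u.reg .r13 = r13) (h_r14 : u.reg .r14 = r14) (h_r15 : u.reg .r15 = r15) (h_rip : u.rip = 0x100000) (h_fl : u.flags = fl) (hμ : μ.vendor = .intel)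
    (hHas : ∀ a n, L.Has a n) (hCan : ∀ a : Word, a < 0x40000000)
    (hNF : ∀ {α : Type} (x : Option α), x ≠ none) (hfam : μ.cfg.field Feature.familyId = 6) (hQ : ∀ v, Q v) :
    InsnGoal L μ u Q (insn% [0x66, 0x8b, 0x43, 0x02]) := by
  u_insn [h_rax, h_rcx, h_rdx, h_rbx, h_rsp, h_rbp, h_rsi, h_rdi, h_r8, h_r9, h_r10, h_r11, h_r12, h_r13, h_r14, h_r15, h_rip, h_fl, hμ]
  all_goals first | exact hHas _ _ | exact hCan _ | exact hNF _ hopt1 | exact Or.inl hfam | exact hQ _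

/-- `mov al, byte ptr [rbx+rcx*1]` -/
example (h_rax : u.reg .rax = rax) (h_rcx : u.reg .rcx = rcx) (h_rdx : u.reg .rdx = rdx) (h_rbx : u.reg .rbx = rbx) (h_rsp : u.reg .rsp = rsp) (h_rbp : u.reg .rbp = rbp) (h_rsi : u.reg .rsi = rsi) (h_rdi : u.reg .rdi = rdi) (h_r8 : u.reg .r8 = r8) (h_r9 : u.reg .r9 = r9) (h_r10 : u.reg .r10 = r10) (h_r11 : u.reg .r11 = r11) (h_r12 : u.reg .r12 = r12) (h_r13 : u.reg .r13 = r13) (h_r14 : u.reg .r14 = r14) (h_r15 : u.reg .r15 = r15) (h_rip : u.rip = 0x100000) (h_fl : u.flags = fl) (hμ : μ.vendor = .intel)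
    (hHas : ∀ a n, L.Has a n) (hCan : ∀ a : Word, a < 0x40000000)
    (hNF : ∀ {α : Type} (x : Option α), x ≠ none) (hfam : μ.cfg.field Feature.familyId = 6) (hQ : ∀ v, Q v) :
    InsnGoal L μ u Q (insn% [0x8a, 0x04, 0x0b]) := by
  u_insn [h_rax, h_rcx, h_rdx, h_rbx, h_rsp, h_rbp, h_rsi, h_rdi, h_r8, h_r9, h_r10, h_r11, h_r12, h_r13, h_r14, h_r15, h_rip, h_fl, hμ]
  all_goals first | exact hHas _ _ | exact hCan _ | exact hNF _ hopt1 | exact Or.inl hfam | exact hQ _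

/-- `mov eax, dword ptr [rbx+rcx*4+0x8]` -/
example (h_rax : u.reg .rax = rax) (h_rcx : u.reg .rcx = rcx) (h_rdx : u.reg .rdx = rdx) (h_rbx : u.reg .rbx = rbx) (h_rsp : u.reg .rsp = rsp) (h_rbp : u.reg .rbp = rbp) (h_rsi : u.reg .rsi = rsi) (h_rdi : u.reg .rdi = rdi) (h_r8 : u.reg .r8 = r8) (h_r9 : u.reg .r9 = r9) (h_r10 : u.reg .r10 = r10) (h_r11 : u.reg .r11 = r11) (h_r12 : u.reg .r12 = r12) (h_r13 : u.reg .r13 = r13) (h_r14 : u.reg .r14 = r14) (h_r15 : u.reg .r15 = r15) (h_rip : u.rip = 0x100000) (h_fl : u.flags = fl) (hμ : μ.vendor = .intel)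
    (hHas : ∀ a n, L.Has a n) (hCan : ∀ a : Word, a < 0x40000000)
    (hNF : ∀ {α : Type} (x : Option α), x ≠ none) (hfam : μ.cfg.field Feature.familyId = 6) (hQ : ∀ v, Q v) :
    InsnGoal L μ u Q (insn% [0x8b, 0x44, 0x8b, 0x08]) := by
  u_insn [h_rax, h_rcx, h_rdx, h_rbx, h_rsp, h_rbp, h_rsi, h_rdi, h_r8, h_r9, h_r10, h_r11, h_r12, h_r13, h_r14, h_r15, h_rip, h_fl, hμ]
  all_goals first | exact hHas _ _ | exact hCan _ | exact hNF _ hopt1 | exact Or.inl hfam | exact hQ _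

/-- `mov rdi, qword ptr ds:0x1ff000` -/
example (h_rax : u.reg .rax = rax) (h_rcx : u.reg .rcx = rcx) (h_rdx : u.reg .rdx = rdx) (h_rbx : u.reg .rbx = rbx) (h_rsp : u.reg .rsp = rsp) (h_rbp : u.reg .rbp = rbp) (h_rsi : u.reg .rsi = rsi) (h_rdi : u.reg .rdi = rdi) (h_r8 : u.reg .r8 = r8) (h_r9 : u.reg .r9 = r9) (h_r10 : u.reg .r10 = r10) (h_r11 : u.reg .r11 = r11) (h_r12 : u.reg .r12 = r12) (h_r13 : u.reg .r13 = r13) (h_r14 : u.reg .r14 = r14) (h_r15 : u.reg .r15 = r15) (h_rip : u.rip = 0x100000) (h_fl : u.flags = fl) (hμ : μ.vendor = .intel)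
    (hHas : ∀ a n, L.Has a n) (hCan : ∀ a : Word, a < 0x40000000)
    (hNF : ∀ {α : Type} (x : Option α), x ≠ none) (hfam : μ.cfg.field Feature.familyId = 6) (hQ : ∀ v, Q v) :
    InsnGoal L μ u Q (insn% [0x48, 0x8b, 0x3c, 0x25, 0x00, 0xf0, 0x1f, 0x00]) := by
  u_insn [h_rax, h_rcx, h_rdx, h_rbx, h_rsp, h_rbp, h_rsi, h_rdi, h_r8, h_r9, h_r10, h_r11, h_r12, h_r13, h_r14, h_r15, h_rip, h_fl, hμ]
  all_goals first | exact hHas _ _ | exact hCan _ | exact hNF _ hopt1 | exact Or.inl hfam | exact hQ _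

/-- `mov rax, qword ptr [rip+0x200]` -/
example (h_rax : u.reg .rax = rax) (h_rcx : u.reg .rcx = rcx) (h_rdx : u.reg .rdx = rdx) (h_rbx : u.reg .rbx = rbx) (h_rsp : u.reg .rsp = rsp) (h_rbp : u.reg .rbp = rbp) (h_rsi : u.reg .rsi = rsi) (h_rdi : u.reg .rdi = rdi) (h_r8 : u.reg .r8 = r8) (h_r9 : u.reg .r9 = r9) (h_r10 : u.reg .r10 = r10) (h_r11 : u.reg .r11 = r11) (h_r12 : u.reg .r12 = r12) (h_r13 : u.reg .r13 = r13) (h_r14 : u.reg .r14 = r14) (h_r15 : u.reg .r15 = r15) (h_rip : u.rip = 0x100000) (h_fl : u.flags = fl) (hμ : μ.vendor = .intel)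
    (hHas : ∀ a n, L.Has a n) (hCan : ∀ a : Word, a < 0x40000000)
    (hNF : ∀ {α : Type} (x : Option α), x ≠ none) (hfam : μ.cfg.field Feature.familyId = 6) (hQ : ∀ v, Q v) :
    InsnGoal L μ u Q (insn% [0x48, 0x8b, 0x05, 0x00, 0x02, 0x00, 0x00]) := by
  u_insn [h_rax, h_rcx, h_rdx, h_rbx, h_rsp, h_rbp, h_rsi, h_rdi, h_r8, h_r9, h_r10, h_r11, h_r12, h_r13, h_r14, h_r15, h_rip, h_fl, hμ]
  all_goals first | exact hHas _ _ | exact hCan _ | exact hNF _ hopt1 | exact Or.inl hfam | exact hQ _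

/-- `mov qword ptr [rsp+0x8], rdi` -/
example (h_rax : u.reg .rax = rax) (h_rcx : u.reg .rcx = rcx) (h_rdx : u.reg .rdx = rdx) (h_rbx : u.reg .rbx = rbx) (h_rsp : u.reg .rsp = rsp) (h_rbp : u.reg .rbp = rbp) (h_rsi : u.reg .rsi = rsi) (h_rdi : u.reg .rdi = rdi) (h_r8 : u.reg .r8 = r8) (h_r9 : u.reg .r9 = r9) (h_r10 : u.reg .r10 = r10) (h_r11 : u.reg .r11 = r11) (h_r12 : u.reg .r12 = r12) (h_r13 : u.reg .r13 = r13) (h_r14 : u.reg .r14 = r14) (h_r15 : u.reg .r15 = r15) (h_rip : u.rip = 0x100000) (h_fl : u.flags = fl) (hμ : μ.vendor = .intel)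
    (hHas : ∀ a n, L.Has a n) (hCan : ∀ a : Word, a < 0x40000000)
    (hNF : ∀ {α : Type} (x : Option α), x ≠ none) (hfam : μ.cfg.field Feature.familyId = 6) (hQ : ∀ v, Q v) :
    InsnGoal L μ u Q (insn% [0x48, 0x89, 0x7c, 0x24, 0x08]) := by
  u_insn [h_rax, h_rcx, h_rdx, h_rbx, h_rsp, h_rbp, h_rsi, h_rdi, h_r8, h_r9, h_r10, h_r11, h_r12, h_r13, h_r14, h_r15, h_rip, h_fl, hμ]
  all_goals first | exact hHas _ _ | exact hCan _ | exact hNF _ hopt1 | exact Or.inl hfam | exact hQ _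

/-- `mov dword ptr [rbp-0xb8], eax` -/
example (h_rax : u.reg .rax = rax) (h_rcx : u.reg .rcx = rcx) (h_rdx : u.reg .rdx = rdx) (h_rbx : u.reg .rbx = rbx) (h_rsp : u.reg .rsp = rsp) (h_rbp : u.reg .rbp = rbp) (h_rsi : u.reg .rsi = rsi) (h_rdi : u.reg .rdi = rdi) (h_r8 : u.reg .r8 = r8) (h_r9 : u.reg .r9 = r9) (h_r10 : u.reg .r10 = r10) (h_r11 : u.reg .r11 = r11) (h_r12 : u.reg .r12 = r12) (h_r13 : u.reg .r13 = r13) (h_r14 : u.reg .r14 = r14) (h_r15 : u.reg .r15 = r15) (h_rip : u.rip = 0x100000) (h_fl : u.flags = fl) (hμ : μ.vendor = .intel)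
    (hHas : ∀ a n, L.Has a n) (hCan : ∀ a : Word, a < 0x40000000)
    (hNF : ∀ {α : Type} (x : Option α), x ≠ none) (hfam : μ.cfg.field Feature.familyId = 6) (hQ : ∀ v, Q v) :
    InsnGoal L μ u Q (insn% [0x89, 0x85, 0x48, 0xff, 0xff, 0xff]) := by
  u_insn [h_rax, h_rcx, h_rdx, h_rbx, h_rsp, h_rbp, h_rsi, h_rdi, h_r8, h_r9, h_r10, h_r11, h_r12, h_r13, h_r14, h_r15, h_rip, h_fl, hμ]
  all_goals first | exact hHas _ _ | exact hCan _ | exact hNF _ hopt1 | exact Or.inl hfam | exact hQ _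

/-- `mov word ptr [rbx], r12w` -/
example (h_rax : u.reg .rax = rax) (h_rcx : u.reg .rcx = rcx) (h_rdx : u.reg .rdx = rdx) (h_rbx : u.reg .rbx = rbx) (h_rsp : u.reg .rsp = rsp) (h_rbp : u.reg .rbp = rbp) (h_rsi : u.reg .rsi = rsi) (h_rdi : u.reg .rdi = rdi) (h_r8 : u.reg .r8 = r8) (h_r9 : u.reg .r9 = r9) (h_r10 : u.reg .r10 = r10) (h_r11 : u.reg .r11 = r11) (h_r12 : u.reg .r12 = r12) (h_r13 : u.reg .r13 = r13) (h_r14 : u.reg .r14 = r14) (h_r15 : u.reg .r15 = r15) (h_rip : u.rip = 0x100000) (h_fl : u.flags = fl) (hμ : μ.vendor = .intel)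
    (hHas : ∀ a n, L.Has a n) (hCan : ∀ a : Word, a < 0x40000000)
    (hNF : ∀ {α : Type} (x : Option α), x ≠ none) (hfam : μ.cfg.field Feature.familyId = 6) (hQ : ∀ v, Q v) :
    InsnGoal L μ u Q (insn% [0x66, 0x44, 0x89, 0x23]) := by
  u_insn [h_rax, h_rcx, h_rdx, h_rbx, h_rsp, h_rbp, h_rsi, h_rdi, h_r8, h_r9, h_r10, h_r11, h_r12, h_r13, h_r14, h_r15, h_rip, h_fl, hμ]
  all_goals first | exact hHas _ _ | exact hCan _ | exact hNF _ hopt1 | exact Or.inl hfam | exact hQ _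

/-- `mov byte ptr [r15], al` -/
example (h_rax : u.reg .rax = rax) (h_rcx : u.reg .rcx = rcx) (h_rdx : u.reg .rdx = rdx) (h_rbx : u.reg .rbx = rbx) (h_rsp : u.reg .rsp = rsp) (h_rbp : u.reg .rbp = rbp) (h_rsi : u.reg .rsi = rsi) (h_rdi : u.reg .rdi = rdi) (h_r8 : u.reg .r8 = r8) (h_r9 : u.reg .r9 = r9) (h_r10 : u.reg .r10 = r10) (h_r11 : u.reg .r11 = r11) (h_r12 : u.reg .r12 = r12) (h_r13 : u.reg .r13 = r13) (h_r14 : u.reg .r14 = r14) (h_r15 : u.reg .r15 = r15) (h_rip : u.rip = 0x100000) (h_fl : u.flags = fl) (hμ : μ.vendor = .intel)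
    (hHas : ∀ a n, L.Has a n) (hCan : ∀ a : Word, a < 0x40000000)
    (hNF : ∀ {α : Type} (x : Option α), x ≠ none) (hfam : μ.cfg.field Feature.familyId = 6) (hQ : ∀ v, Q v) :
    InsnGoal L μ u Q (insn% [0x41, 0x88, 0x07]) := by
  u_insn [h_rax, h_rcx, h_rdx, h_rbx, h_rsp, h_rbp, h_rsi, h_rdi, h_r8, h_r9, h_r10, h_r11, h_r12, h_r13, h_r14, h_r15, h_rip, h_fl, hμ]
  all_goals first | exact hHas _ _ | exact hCan _ | exact hNF _ hopt1 | exact Or.inl hfam | exact hQ _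

/-- `mov qword ptr [rsp+0x30], 0x41b58ab3` -/
example (h_rax : u.reg .rax = rax) (h_rcx : u.reg .rcx = rcx) (h_rdx : u.reg .rdx = rdx) (h_rbx : u.reg .rbx = rbx) (h_rsp : u.reg .rsp = rsp) (h_rbp : u.reg .rbp = rbp) (h_rsi : u.reg .rsi = rsi) (h_rdi : u.reg .rdi = rdi) (h_r8 : u.reg .r8 = r8) (h_r9 : u.reg .r9 = r9) (h_r10 : u.reg .r10 = r10) (h_r11 : u.reg .r11 = r11) (h_r12 : u.reg .r12 = r12) (h_r13 : u.reg .r13 = r13) (h_r14 : u.reg .r14 = r14) (h_r15 : u.reg .r15 = r15) (h_rip : u.rip = 0x100000) (h_fl : u.flags = fl) (hμ : μ.vendor = .intel)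
    (hHas : ∀ a n, L.Has a n) (hCan : ∀ a : Word, a < 0x40000000)
    (hNF : ∀ {α : Type} (x : Option α), x ≠ none) (hfam : μ.cfg.field Feature.familyId = 6) (hQ : ∀ v, Q v) :
    InsnGoal L μ u Q (insn% [0x48, 0xc7, 0x44, 0x24, 0x30, 0xb3, 0x8a, 0xb5, 0x41]) := by
  u_insn [h_rax, h_rcx, h_rdx, h_rbx, h_rsp, h_rbp, h_rsi, h_rdi, h_r8, h_r9, h_r10, h_r11, h_r12, h_r13, h_r14, h_r15, h_rip, h_fl, hμ]
  all_goals first | exact hHas _ _ | exact hCan _ | exact hNF _ hopt1 | exact Or.inl hfam | exact hQ _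

/-- `mov dword ptr [rbx+0xc00000], 0xf1f1f1f1` -/
example (h_rax : u.reg .rax = rax) (h_rcx : u.reg .rcx = rcx) (h_rdx : u.reg .rdx = rdx) (h_rbx : u.reg .rbx = rbx) (h_rsp : u.reg .rsp = rsp) (h_rbp : u.reg .rbp = rbp) (h_rsi : u.reg .rsi = rsi) (h_rdi : u.reg .rdi = rdi) (h_r8 : u.reg .r8 = r8) (h_r9 : u.reg .r9 = r9) (h_r10 : u.reg .r10 = r10) (h_r11 : u.reg .r11 = r11) (h_r12 : u.reg .r12 = r12) (h_r13 : u.reg .r13 = r13) (h_r14 : u.reg .r14 = r14) (h_r15 : u.reg .r15 = r15) (h_rip : u.rip = 0x100000) (h_fl : u.flags = fl) (hμ : μ.vendor = .intel)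
    (hHas : ∀ a n, L.Has a n) (hCan : ∀ a : Word, a < 0x40000000)
    (hNF : ∀ {α : Type} (x : Option α), x ≠ none) (hfam : μ.cfg.field Feature.familyId = 6) (hQ : ∀ v, Q v) :
    InsnGoal L μ u Q (insn% [0xc7, 0x83, 0x00, 0x00, 0xc0, 0x00, 0xf1, 0xf1, 0xf1, 0xf1]) := by
  u_insn [h_rax, h_rcx, h_rdx, h_rbx, h_rsp, h_rbp, h_rsi, h_rdi, h_r8, h_r9, h_r10, h_r11, h_r12, h_r13, h_r14, h_r15, h_rip, h_fl, hμ]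
  all_goals first | exact hHas _ _ | exact hCan _ | exact hNF _ hopt1 | exact Or.inl hfam | exact hQ _

/-- `mov word ptr [rbx+0x152], 0x0` -/
example (h_rax : u.reg .rax = rax) (h_rcx : u.reg .rcx = rcx) (h_rdx : u.reg .rdx = rdx) (h_rbx : u.reg .rbx = rbx) (h_rsp : u.reg .rsp = rsp) (h_rbp : u.reg .rbp = rbp) (h_rsi : u.reg .rsi = rsi) (h_rdi : u.reg .rdi = rdi) (h_r8 : u.reg .r8 = r8) (h_r9 : u.reg .r9 = r9) (h_r10 : u.reg .r10 = r10) (h_r11 : u.reg .r11 = r11) (h_r12 : u.reg .r12 = r12) (h_r13 : u.reg .r13 = r13) (h_r14 : u.reg .r14 = r14) (h_r15 : u.reg .r15 = r15) (h_rip : u.rip = 0x100000) (h_fl : u.flags = fl) (hμ : μ.vendor = .intel)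
    (hHas : ∀ a n, L.Has a n) (hCan : ∀ a : Word, a < 0x40000000)
    (hNF : ∀ {α : Type} (x : Option α), x ≠ none) (hfam : μ.cfg.field Feature.familyId = 6) (hQ : ∀ v, Q v) :
    InsnGoal L μ u Q (insn% [0x66, 0xc7, 0x83, 0x52, 0x01, 0x00, 0x00, 0x00, 0x00]) := by
  u_insn [h_rax, h_rcx, h_rdx, h_rbx, h_rsp, h_rbp, h_rsi, h_rdi, h_r8, h_r9, h_r10, h_r11, h_r12, h_r13, h_r14, h_r15, h_rip, h_fl, hμ]
  all_goals first | exact hHas _ _ | exact hCan _ | exact hNF _ hopt1 | exact Or.inl hfam | exact hQ _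

/-- `mov byte ptr [rdi+0xc00000], 0xfa` -/
example (h_rax : u.reg .rax = rax) (h_rcx : u.reg .rcx = rcx) (h_rdx : u.reg .rdx = rdx) (h_rbx : u.reg .rbx = rbx) (h_rsp : u.reg .rsp = rsp) (h_rbp : u.reg .rbp = rbp) (h_rsi : u.reg .rsi = rsi) (h_rdi : u.reg .rdi = rdi) (h_r8 : u.reg .r8 = r8) (h_r9 : u.reg .r9 = r9) (h_r10 : u.reg .r10 = r10) (h_r11 : u.reg .r11 = r11) (h_r12 : u.reg .r12 = r12) (h_r13 : u.reg .r13 = r13) (h_r14 : u.reg .r14 = r14) (h_r15 : u.reg .r15 = r15) (h_rip : u.rip = 0x100000) (h_fl : u.flags = fl) (hμ : μ.vendor = .intel)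
    (hHas : ∀ a n, L.Has a n) (hCan : ∀ a : Word, a < 0x40000000)
    (hNF : ∀ {α : Type} (x : Option α), x ≠ none) (hfam : μ.cfg.field Feature.familyId = 6) (hQ : ∀ v, Q v) :
    InsnGoal L μ u Q (insn% [0xc6, 0x87, 0x00, 0x00, 0xc0, 0x00, 0xfa]) := by
  u_insn [h_rax, h_rcx, h_rdx, h_rbx, h_rsp, h_rbp, h_rsi, h_rdi, h_r8, h_r9, h_r10, h_r11, h_r12, h_r13, h_r14, h_r15, h_rip, h_fl, hμ]
  all_goals first | exact hHas _ _ | exact hCan _ | exact hNF _ hopt1 | exact Or.inl hfam | exact hQ _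

/-- `movzx eax, al` -/
example (h_rax : u.reg .rax = rax) (h_rcx : u.reg .rcx = rcx) (h_rdx : u.reg .rdx = rdx) (h_rbx : u.reg .rbx = rbx) (h_rsp : u.reg .rsp = rsp) (h_rbp : u.reg .rbp = rbp) (h_rsi : u.reg .rsi = rsi) (h_rdi : u.reg .rdi = rdi) (h_r8 : u.reg .r8 = r8) (h_r9 : u.reg .r9 = r9) (h_r10 : u.reg .r10 = r10) (h_r11 : u.reg .r11 = r11) (h_r12 : u.reg .r12 = r12) (h_r13 : u.reg .r13 = r13) (h_r14 : u.reg .r14 = r14) (h_r15 : u.reg .r15 = r15) (h_rip : u.rip = 0x100000) (h_fl : u.flags = fl) (hμ : μ.vendor = .intel)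
    (hHas : ∀ a n, L.Has a n) (hCan : ∀ a : Word, a < 0x40000000)
    (hNF : ∀ {α : Type} (x : Option α), x ≠ none) (hfam : μ.cfg.field Feature.familyId = 6) (hQ : ∀ v, Q v) :
    InsnGoal L μ u Q (insn% [0x0f, 0xb6, 0xc0]) := by
  u_insn [h_rax, h_rcx, h_rdx, h_rbx, h_rsp, h_rbp, h_rsi, h_rdi, h_r8, h_r9, h_r10, h_r11, h_r12, h_r13, h_r14, h_r15, h_rip, h_fl, hμ]
  all_goals first | exact hHas _ _ | exact hCan _ | exact hNF _ hopt1 | exact Or.inl hfam | exact hQ _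

/-- `movzx edx, byte ptr [rdx+0xc00000]` -/
example (h_rax : u.reg .rax = rax) (h_rcx : u.reg .rcx = rcx) (h_rdx : u.reg .rdx = rdx) (h_rbx : u.reg .rbx = rbx) (h_rsp : u.reg .rsp = rsp) (h_rbp : u.reg .rbp = rbp) (h_rsi : u.reg .rsi = rsi) (h_rdi : u.reg .rdi = rdi) (h_r8 : u.reg .r8 = r8) (h_r9 : u.reg .r9 = r9) (h_r10 : u.reg .r10 = r10) (h_r11 : u.reg .r11 = r11) (h_r12 : u.reg .r12 = r12) (h_r13 : u.reg .r13 = r13) (h_r14 : u.reg .r14 = r14) (h_r15 : u.reg .r15 = r15) (h_rip : u.rip = 0x100000) (h_fl : u.flags = fl) (hμ : μ.vendor = .intel)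
    (hHas : ∀ a n, L.Has a n) (hCan : ∀ a : Word, a < 0x40000000)
    (hNF : ∀ {α : Type} (x : Option α), x ≠ none) (hfam : μ.cfg.field Feature.familyId = 6) (hQ : ∀ v, Q v) :
    InsnGoal L μ u Q (insn% [0x0f, 0xb6, 0x92, 0x00, 0x00, 0xc0, 0x00]) := by
  u_insn [h_rax, h_rcx, h_rdx, h_rbx, h_rsp, h_rbp, h_rsi, h_rdi, h_r8, h_r9, h_r10, h_r11, h_r12, h_r13, h_r14, h_r15, h_rip, h_fl, hμ]
  all_goals first | exact hHas _ _ | exact hCan _ | exact hNF _ hopt1 | exact Or.inl hfam | exact hQ _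

/-- `movzx eax, cx` -/
example (h_rax : u.reg .rax = rax) (h_rcx : u.reg .rcx = rcx) (h_rdx : u.reg .rdx = rdx) (h_rbx : u.reg .rbx = rbx) (h_rsp : u.reg .rsp = rsp) (h_rbp : u.reg .rbp = rbp) (h_rsi : u.reg .rsi = rsi) (h_rdi : u.reg .rdi = rdi) (h_r8 : u.reg .r8 = r8) (h_r9 : u.reg .r9 = r9) (h_r10 : u.reg .r10 = r10) (h_r11 : u.reg .r11 = r11) (h_r12 : u.reg .r12 = r12) (h_r13 : u.reg .r13 = r13) (h_r14 : u.reg .r14 = r14) (h_r15 : u.reg .r15 = r15) (h_rip : u.rip = 0x100000) (h_fl : u.flags = fl) (hμ : μ.vendor = .intel)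
    (hHas : ∀ a n, L.Has a n) (hCan : ∀ a : Word, a < 0x40000000)
    (hNF : ∀ {α : Type} (x : Option α), x ≠ none) (hfam : μ.cfg.field Feature.familyId = 6) (hQ : ∀ v, Q v) :
    InsnGoal L μ u Q (insn% [0x0f, 0xb7, 0xc1]) := by
  u_insn [h_rax, h_rcx, h_rdx, h_rbx, h_rsp, h_rbp, h_rsi, h_rdi, h_r8, h_r9, h_r10, h_r11, h_r12, h_r13, h_r14, h_r15, h_rip, h_fl, hμ]
  all_goals first | exact hHas _ _ | exact hCan _ | exact hNF _ hopt1 | exact Or.inl hfam | exact hQ _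

/-- `movzx eax, word ptr [rbx+4]` -/
example (h_rax : u.reg .rax = rax) (h_rcx : u.reg .rcx = rcx) (h_rdx : u.reg .rdx = rdx) (h_rbx : u.reg .rbx = rbx) (h_rsp : u.reg .rsp = rsp) (h_rbp : u.reg .rbp = rbp) (h_rsi : u.reg .rsi = rsi) (h_rdi : u.reg .rdi = rdi) (h_r8 : u.reg .r8 = r8) (h_r9 : u.reg .r9 = r9) (h_r10 : u.reg .r10 = r10) (h_r11 : u.reg .r11 = r11) (h_r12 : u.reg .r12 = r12) (h_r13 : u.reg .r13 = r13) (h_r14 : u.reg .r14 = r14) (h_r15 : u.reg .r15 = r15) (h_rip : u.rip = 0x100000) (h_fl : u.flags = fl) (hμ : μ.vendor = .intel)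
    (hHas : ∀ a n, L.Has a n) (hCan : ∀ a : Word, a < 0x40000000)
    (hNF : ∀ {α : Type} (x : Option α), x ≠ none) (hfam : μ.cfg.field Feature.familyId = 6) (hQ : ∀ v, Q v) :
    InsnGoal L μ u Q (insn% [0x0f, 0xb7, 0x43, 0x04]) := by
  u_insn [h_rax, h_rcx, h_rdx, h_rbx, h_rsp, h_rbp, h_rsi, h_rdi, h_r8, h_r9, h_r10, h_r11, h_r12, h_r13, h_r14, h_r15, h_rip, h_fl, hμ]
  all_goals first | exact hHas _ _ | exact hCan _ | exact hNF _ hopt1 | exact Or.inl hfam | exact hQ _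

/-- `movsx eax, byte ptr [rbx+0x1202a0]` -/
example (h_rax : u.reg .rax = rax) (h_rcx : u.reg .rcx = rcx) (h_rdx : u.reg .rdx = rdx) (h_rbx : u.reg .rbx = rbx) (h_rsp : u.reg .rsp = rsp) (h_rbp : u.reg .rbp = rbp) (h_rsi : u.reg .rsi = rsi) (h_rdi : u.reg .rdi = rdi) (h_r8 : u.reg .r8 = r8) (h_r9 : u.reg .r9 = r9) (h_r10 : u.reg .r10 = r10) (h_r11 : u.reg .r11 = r11) (h_r12 : u.reg .r12 = r12) (h_r13 : u.reg .r13 = r13) (h_r14 : u.reg .r14 = r14) (h_r15 : u.reg .r15 = r15) (h_rip : u.rip = 0x100000) (h_fl : u.flags = fl) (hμ : μ.vendor = .intel)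
    (hHas : ∀ a n, L.Has a n) (hCan : ∀ a : Word, a < 0x40000000)
    (hNF : ∀ {α : Type} (x : Option α), x ≠ none) (hfam : μ.cfg.field Feature.familyId = 6) (hQ : ∀ v, Q v) :
    InsnGoal L μ u Q (insn% [0x0f, 0xbe, 0x83, 0xa0, 0x02, 0x12, 0x00]) := by
  u_insn [h_rax, h_rcx, h_rdx, h_rbx, h_rsp, h_rbp, h_rsi, h_rdi, h_r8, h_r9, h_r10, h_r11, h_r12, h_r13, h_r14, h_r15, h_rip, h_fl, hμ]
  all_goals first | exact hHas _ _ | exact hCan _ | exact hNF _ hopt1 | exact Or.inl hfam | exact hQ _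

/-- `movsx rbx, bx` -/
example (h_rax : u.reg .rax = rax) (h_rcx : u.reg .rcx = rcx) (h_rdx : u.reg .rdx = rdx) (h_rbx : u.reg .rbx = rbx) (h_rsp : u.reg .rsp = rsp) (h_rbp : u.reg .rbp = rbp) (h_rsi : u.reg .rsi = rsi) (h_rdi : u.reg .rdi = rdi) (h_r8 : u.reg .r8 = r8) (h_r9 : u.reg .r9 = r9) (h_r10 : u.reg .r10 = r10) (h_r11 : u.reg .r11 = r11) (h_r12 : u.reg .r12 = r12) (h_r13 : u.reg .r13 = r13) (h_r14 : u.reg .r14 = r14) (h_r15 : u.reg .r15 = r15) (h_rip : u.rip = 0x100000) (h_fl : u.flags = fl) (hμ : μ.vendor = .intel)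
    (hHas : ∀ a n, L.Has a n) (hCan : ∀ a : Word, a < 0x40000000)
    (hNF : ∀ {α : Type} (x : Option α), x ≠ none) (hfam : μ.cfg.field Feature.familyId = 6) (hQ : ∀ v, Q v) :
    InsnGoal L μ u Q (insn% [0x48, 0x0f, 0xbf, 0xdb]) := by
  u_insn [h_rax, h_rcx, h_rdx, h_rbx, h_rsp, h_rbp, h_rsi, h_rdi, h_r8, h_r9, h_r10, h_r11, h_r12, h_r13, h_r14, h_r15, h_rip, h_fl, hμ]
  all_goals first | exact hHas _ _ | exact hCan _ | exact hNF _ hopt1 | exact Or.inl hfam | exact hQ _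

/-- `movsx eax, cl` -/
example (h_rax : u.reg .rax = rax) (h_rcx : u.reg .rcx = rcx) (h_rdx : u.reg .rdx = rdx) (h_rbx : u.reg .rbx = rbx) (h_rsp : u.reg .rsp = rsp) (h_rbp : u.reg .rbp = rbp) (h_rsi : u.reg .rsi = rsi) (h_rdi : u.reg .rdi = rdi) (h_r8 : u.reg .r8 = r8) (h_r9 : u.reg .r9 = r9) (h_r10 : u.reg .r10 = r10) (h_r11 : u.reg .r11 = r11) (h_r12 : u.reg .r12 = r12) (h_r13 : u.reg .r13 = r13) (h_r14 : u.reg .r14 = r14) (h_r15 : u.reg .r15 = r15) (h_rip : u.rip = 0x100000) (h_fl : u.flags = fl) (hμ : μ.vendor = .intel)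
    (hHas : ∀ a n, L.Has a n) (hCan : ∀ a : Word, a < 0x40000000)
    (hNF : ∀ {α : Type} (x : Option α), x ≠ none) (hfam : μ.cfg.field Feature.familyId = 6) (hQ : ∀ v, Q v) :
    InsnGoal L μ u Q (insn% [0x0f, 0xbe, 0xc1]) := by
  u_insn [h_rax, h_rcx, h_rdx, h_rbx, h_rsp, h_rbp, h_rsi, h_rdi, h_r8, h_r9, h_r10, h_r11, h_r12, h_r13, h_r14, h_r15, h_rip, h_fl, hμ]
  all_goals first | exact hHas _ _ | exact hCan _ | exact hNF _ hopt1 | exact Or.inl hfam | exact hQ _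

/-- `movsxd rax, ebx` -/
example (h_rax : u.reg .rax = rax) (h_rcx : u.reg .rcx = rcx) (h_rdx : u.reg .rdx = rdx) (h_rbx : u.reg .rbx = rbx) (h_rsp : u.reg .rsp = rsp) (h_rbp : u.reg .rbp = rbp) (h_rsi : u.reg .rsi = rsi) (h_rdi : u.reg .rdi = rdi) (h_r8 : u.reg .r8 = r8) (h_r9 : u.reg .r9 = r9) (h_r10 : u.reg .r10 = r10) (h_r11 : u.reg .r11 = r11) (h_r12 : u.reg .r12 = r12) (h_r13 : u.reg .r13 = r13) (h_r14 : u.reg .r14 = r14) (h_r15 : u.reg .r15 = r15) (h_rip : u.rip = 0x100000) (h_fl : u.flags = fl) (hμ : μ.vendor = .intel)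
    (hHas : ∀ a n, L.Has a n) (hCan : ∀ a : Word, a < 0x40000000)
    (hNF : ∀ {α : Type} (x : Option α), x ≠ none) (hfam : μ.cfg.field Feature.familyId = 6) (hQ : ∀ v, Q v) :
    InsnGoal L μ u Q (insn% [0x48, 0x63, 0xc3]) := by
  u_insn [h_rax, h_rcx, h_rdx, h_rbx, h_rsp, h_rbp, h_rsi, h_rdi, h_r8, h_r9, h_r10, h_r11, h_r12, h_r13, h_r14, h_r15, h_rip, h_fl, hμ]
  all_goals first | exact hHas _ _ | exact hCan _ | exact hNF _ hopt1 | exact Or.inl hfam | exact hQ _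

/-- `movsxd rax, dword ptr [rsp+0x10]` -/
example (h_rax : u.reg .rax = rax) (h_rcx : u.reg .rcx = rcx) (h_rdx : u.reg .rdx = rdx) (h_rbx : u.reg .rbx = rbx) (h_rsp : u.reg .rsp = rsp) (h_rbp : u.reg .rbp = rbp) (h_rsi : u.reg .rsi = rsi) (h_rdi : u.reg .rdi = rdi) (h_r8 : u.reg .r8 = r8) (h_r9 : u.reg .r9 = r9) (h_r10 : u.reg .r10 = r10) (h_r11 : u.reg .r11 = r11) (h_r12 : u.reg .r12 = r12) (h_r13 : u.reg .r13 = r13) (h_r14 : u.reg .r14 = r14) (h_r15 : u.reg .r15 = r15) (h_rip : u.rip = 0x100000) (h_fl : u.flags = fl) (hμ : μ.vendor = .intel)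
    (hHas : ∀ a n, L.Has a n) (hCan : ∀ a : Word, a < 0x40000000)
    (hNF : ∀ {α : Type} (x : Option α), x ≠ none) (hfam : μ.cfg.field Feature.familyId = 6) (hQ : ∀ v, Q v) :
    InsnGoal L μ u Q (insn% [0x48, 0x63, 0x44, 0x24, 0x10]) := by
  u_insn [h_rax, h_rcx, h_rdx, h_rbx, h_rsp, h_rbp, h_rsi, h_rdi, h_r8, h_r9, h_r10, h_r11, h_r12, h_r13, h_r14, h_r15, h_rip, h_fl, hμ]
  all_goals first | exact hHas _ _ | exact hCan _ | exact hNF _ hopt1 | exact Or.inl hfam | exact hQ _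

/-- `lea rdi, [rbx+0x4]` -/
example (h_rax : u.reg .rax = rax) (h_rcx : u.reg .rcx = rcx) (h_rdx : u.reg .rdx = rdx) (h_rbx : u.reg .rbx = rbx) (h_rsp : u.reg .rsp = rsp) (h_rbp : u.reg .rbp = rbp) (h_rsi : u.reg .rsi = rsi) (h_rdi : u.reg .rdi = rdi) (h_r8 : u.reg .r8 = r8) (h_r9 : u.reg .r9 = r9) (h_r10 : u.reg .r10 = r10) (h_r11 : u.reg .r11 = r11) (h_r12 : u.reg .r12 = r12) (h_r13 : u.reg .r13 = r13) (h_r14 : u.reg .r14 = r14) (h_r15 : u.reg .r15 = r15) (h_rip : u.rip = 0x100000) (h_fl : u.flags = fl) (hμ : μ.vendor = .intel)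
    (hHas : ∀ a n, L.Has a n) (hCan : ∀ a : Word, a < 0x40000000)
    (hNF : ∀ {α : Type} (x : Option α), x ≠ none) (hfam : μ.cfg.field Feature.familyId = 6) (hQ : ∀ v, Q v) :
    InsnGoal L μ u Q (insn% [0x48, 0x8d, 0x7b, 0x04]) := by
  u_insn [h_rax, h_rcx, h_rdx, h_rbx, h_rsp, h_rbp, h_rsi, h_rdi, h_r8, h_r9, h_r10, h_r11, h_r12, h_r13, h_r14, h_r15, h_rip, h_fl, hμ]
  all_goals first | exact hHas _ _ | exact hCan _ | exact hNF _ hopt1 | exact Or.inl hfam | exact hQ _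

/-- `lea rbx, [rdx+rax*4]` -/
example (h_rax : u.reg .rax = rax) (h_rcx : u.reg .rcx = rcx) (h_rdx : u.reg .rdx = rdx) (h_rbx : u.reg .rbx = rbx) (h_rsp : u.reg .rsp = rsp) (h_rbp : u.reg .rbp = rbp) (h_rsi : u.reg .rsi = rsi) (h_rdi : u.reg .rdi = rdi) (h_r8 : u.reg .r8 = r8) (h_r9 : u.reg .r9 = r9) (h_r10 : u.reg .r10 = r10) (h_r11 : u.reg .r11 = r11) (h_r12 : u.reg .r12 = r12) (h_r13 : u.reg .r13 = r13) (h_r14 : u.reg .r14 = r14) (h_r15 : u.reg .r15 = r15) (h_rip : u.rip = 0x100000) (h_fl : u.flags = fl) (hμ : μ.vendor = .intel)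
    (hHas : ∀ a n, L.Has a n) (hCan : ∀ a : Word, a < 0x40000000)
    (hNF : ∀ {α : Type} (x : Option α), x ≠ none) (hfam : μ.cfg.field Feature.familyId = 6) (hQ : ∀ v, Q v) :
    InsnGoal L μ u Q (insn% [0x48, 0x8d, 0x1c, 0x82]) := by
  u_insn [h_rax, h_rcx, h_rdx, h_rbx, h_rsp, h_rbp, h_rsi, h_rdi, h_r8, h_r9, h_r10, h_r11, h_r12, h_r13, h_r14, h_r15, h_rip, h_fl, hμ]
  all_goals first | exact hHas _ _ | exact hCan _ | exact hNF _ hopt1 | exact Or.inl hfam | exact hQ _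

/-- `lea rdi, [rsp+r14*4+0x280]` -/
example (h_rax : u.reg .rax = rax) (h_rcx : u.reg .rcx = rcx) (h_rdx : u.reg .rdx = rdx) (h_rbx : u.reg .rbx = rbx) (h_rsp : u.reg .rsp = rsp) (h_rbp : u.reg .rbp = rbp) (h_rsi : u.reg .rsi = rsi) (h_rdi : u.reg .rdi = rdi) (h_r8 : u.reg .r8 = r8) (h_r9 : u.reg .r9 = r9) (h_r10 : u.reg .r10 = r10) (h_r11 : u.reg .r11 = r11) (h_r12 : u.reg .r12 = r12) (h_r13 : u.reg .r13 = r13) (h_r14 : u.reg .r14 = r14) (h_r15 : u.reg .r15 = r15) (h_rip : u.rip = 0x100000) (h_fl : u.flags = fl) (hμ : μ.vendor = .intel)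
    (hHas : ∀ a n, L.Has a n) (hCan : ∀ a : Word, a < 0x40000000)
    (hNF : ∀ {α : Type} (x : Option α), x ≠ none) (hfam : μ.cfg.field Feature.familyId = 6) (hQ : ∀ v, Q v) :
    InsnGoal L μ u Q (insn% [0x4a, 0x8d, 0xbc, 0xb4, 0x80, 0x02, 0x00, 0x00]) := by
  u_insn [h_rax, h_rcx, h_rdx, h_rbx, h_rsp, h_rbp, h_rsi, h_rdi, h_r8, h_r9, h_r10, h_r11, h_r12, h_r13, h_r14, h_r15, h_rip, h_fl, hμ]
  all_goals first | exact hHas _ _ | exact hCan _ | exact hNF _ hopt1 | exact Or.inl hfam | exact hQ _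

/-- `lea esi, [rax*4+0x0]` -/
example (h_rax : u.reg .rax = rax) (h_rcx : u.reg .rcx = rcx) (h_rdx : u.reg .rdx = rdx) (h_rbx : u.reg .rbx = rbx) (h_rsp : u.reg .rsp = rsp) (h_rbp : u.reg .rbp = rbp) (h_rsi : u.reg .rsi = rsi) (h_rdi : u.reg .rdi = rdi) (h_r8 : u.reg .r8 = r8) (h_r9 : u.reg .r9 = r9) (h_r10 : u.reg .r10 = r10) (h_r11 : u.reg .r11 = r11) (h_r12 : u.reg .r12 = r12) (h_r13 : u.reg .r13 = r13) (h_r14 : u.reg .r14 = r14) (h_r15 : u.reg .r15 = r15) (h_rip : u.rip = 0x100000) (h_fl : u.flags = fl) (hμ : μ.vendor = .intel)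
    (hHas : ∀ a n, L.Has a n) (hCan : ∀ a : Word, a < 0x40000000)
    (hNF : ∀ {α : Type} (x : Option α), x ≠ none) (hfam : μ.cfg.field Feature.familyId = 6) (hQ : ∀ v, Q v) :
    InsnGoal L μ u Q (insn% [0x8d, 0x34, 0x85, 0x00, 0x00, 0x00, 0x00]) := by
  u_insn [h_rax, h_rcx, h_rdx, h_rbx, h_rsp, h_rbp, h_rsi, h_rdi, h_r8, h_r9, h_r10, h_r11, h_r12, h_r13, h_r14, h_r15, h_rip, h_fl, hμ]
  all_goals first | exact hHas _ _ | exact hCan _ | exact hNF _ hopt1 | exact Or.inl hfam | exact hQ _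

/-- `lea rax, [rip+0x1234]` -/
example (h_rax : u.reg .rax = rax) (h_rcx : u.reg .rcx = rcx) (h_rdx : u.reg .rdx = rdx) (h_rbx : u.reg .rbx = rbx) (h_rsp : u.reg .rsp = rsp) (h_rbp : u.reg .rbp = rbp) (h_rsi : u.reg .rsi = rsi) (h_rdi : u.reg .rdi = rdi) (h_r8 : u.reg .r8 = r8) (h_r9 : u.reg .r9 = r9) (h_r10 : u.reg .r10 = r10) (h_r11 : u.reg .r11 = r11) (h_r12 : u.reg .r12 = r12) (h_r13 : u.reg .r13 = r13) (h_r14 : u.reg .r14 = r14) (h_r15 : u.reg .r15 = r15) (h_rip : u.rip = 0x100000) (h_fl : u.flags = fl) (hμ : μ.vendor = .intel)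
    (hHas : ∀ a n, L.Has a n) (hCan : ∀ a : Word, a < 0x40000000)
    (hNF : ∀ {α : Type} (x : Option α), x ≠ none) (hfam : μ.cfg.field Feature.familyId = 6) (hQ : ∀ v, Q v) :
    InsnGoal L μ u Q (insn% [0x48, 0x8d, 0x05, 0x34, 0x12, 0x00, 0x00]) := by
  u_insn [h_rax, h_rcx, h_rdx, h_rbx, h_rsp, h_rbp, h_rsi, h_rdi, h_r8, h_r9, h_r10, h_r11, h_r12, h_r13, h_r14, h_r15, h_rip, h_fl, hμ]
  all_goals first | exact hHas _ _ | exact hCan _ | exact hNF _ hopt1 | exact Or.inl hfam | exact hQ _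

/-- `lea eax, [rdi+rsi*1]` -/
example (h_rax : u.reg .rax = rax) (h_rcx : u.reg .rcx = rcx) (h_rdx : u.reg .rdx = rdx) (h_rbx : u.reg .rbx = rbx) (h_rsp : u.reg .rsp = rsp) (h_rbp : u.reg .rbp = rbp) (h_rsi : u.reg .rsi = rsi) (h_rdi : u.reg .rdi = rdi) (h_r8 : u.reg .r8 = r8) (h_r9 : u.reg .r9 = r9) (h_r10 : u.reg .r10 = r10) (h_r11 : u.reg .r11 = r11) (h_r12 : u.reg .r12 = r12) (h_r13 : u.reg .r13 = r13) (h_r14 : u.reg .r14 = r14) (h_r15 : u.reg .r15 = r15) (h_rip : u.rip = 0x100000) (h_fl : u.flags = fl) (hμ : μ.vendor = .intel)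
    (hHas : ∀ a n, L.Has a n) (hCan : ∀ a : Word, a < 0x40000000)
    (hNF : ∀ {α : Type} (x : Option α), x ≠ none) (hfam : μ.cfg.field Feature.familyId = 6) (hQ : ∀ v, Q v) :
    InsnGoal L μ u Q (insn% [0x8d, 0x04, 0x37]) := by
  u_insn [h_rax, h_rcx, h_rdx, h_rbx, h_rsp, h_rbp, h_rsi, h_rdi, h_r8, h_r9, h_r10, h_r11, h_r12, h_r13, h_r14, h_r15, h_rip, h_fl, hμ]
  all_goals first | exact hHas _ _ | exact hCan _ | exact hNF _ hopt1 | exact Or.inl hfam | exact hQ _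

/-- `add rsp, 0x8` -/
example (h_rax : u.reg .rax = rax) (h_rcx : u.reg .rcx = rcx) (h_rdx : u.reg .rdx = rdx) (h_rbx : u.reg .rbx = rbx) (h_rsp : u.reg .rsp = rsp) (h_rbp : u.reg .rbp = rbp) (h_rsi : u.reg .rsi = rsi) (h_rdi : u.reg .rdi = rdi) (h_r8 : u.reg .r8 = r8) (h_r9 : u.reg .r9 = r9) (h_r10 : u.reg .r10 = r10) (h_r11 : u.reg .r11 = r11) (h_r12 : u.reg .r12 = r12) (h_r13 : u.reg .r13 = r13) (h_r14 : u.reg .r14 = r14) (h_r15 : u.reg .r15 = r15) (h_rip : u.rip = 0x100000) (h_fl : u.flags = fl) (hμ : μ.vendor = .intel)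
    (hHas : ∀ a n, L.Has a n) (hCan : ∀ a : Word, a < 0x40000000)
    (hNF : ∀ {α : Type} (x : Option α), x ≠ none) (hfam : μ.cfg.field Feature.familyId = 6) (hQ : ∀ v, Q v) :
    InsnGoal L μ u Q (insn% [0x48, 0x83, 0xc4, 0x08]) := by
  u_insn [h_rax, h_rcx, h_rdx, h_rbx, h_rsp, h_rbp, h_rsi, h_rdi, h_r8, h_r9, h_r10, h_r11, h_r12, h_r13, h_r14, h_r15, h_rip, h_fl, hμ]
  all_goals first | exact hHas _ _ | exact hCan _ | exact hNF _ hopt1 | exact Or.inl hfam | exact hQ _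

/-- `add r12d, 0x1` -/
example (h_rax : u.reg .rax = rax) (h_rcx : u.reg .rcx = rcx) (h_rdx : u.reg .rdx = rdx) (h_rbx : u.reg .rbx = rbx) (h_rsp : u.reg .rsp = rsp) (h_rbp : u.reg .rbp = rbp) (h_rsi : u.reg .rsi = rsi) (h_rdi : u.reg .rdi = rdi) (h_r8 : u.reg .r8 = r8) (h_r9 : u.reg .r9 = r9) (h_r10 : u.reg .r10 = r10) (h_r11 : u.reg .r11 = r11) (h_r12 : u.reg .r12 = r12) (h_r13 : u.reg .r13 = r13) (h_r14 : u.reg .r14 = r14) (h_r15 : u.reg .r15 = r15) (h_rip : u.rip = 0x100000) (h_fl : u.flags = fl) (hμ : μ.vendor = .intel)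
    (hHas : ∀ a n, L.Has a n) (hCan : ∀ a : Word, a < 0x40000000)
    (hNF : ∀ {α : Type} (x : Option α), x ≠ none) (hfam : μ.cfg.field Feature.familyId = 6) (hQ : ∀ v, Q v) :
    InsnGoal L μ u Q (insn% [0x41, 0x83, 0xc4, 0x01]) := by
  u_insn [h_rax, h_rcx, h_rdx, h_rbx, h_rsp, h_rbp, h_rsi, h_rdi, h_r8, h_r9, h_r10, h_r11, h_r12, h_r13, h_r14, h_r15, h_rip, h_fl, hμ]
  all_goals first | exact hHas _ _ | exact hCan _ | exact hNF _ hopt1 | exact Or.inl hfam | exact hQ _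

/-- `add rax, rbx` -/
example (h_rax : u.reg .rax = rax) (h_rcx : u.reg .rcx = rcx) (h_rdx : u.reg .rdx = rdx) (h_rbx : u.reg .rbx = rbx) (h_rsp : u.reg .rsp = rsp) (h_rbp : u.reg .rbp = rbp) (h_rsi : u.reg .rsi = rsi) (h_rdi : u.reg .rdi = rdi) (h_r8 : u.reg .r8 = r8) (h_r9 : u.reg .r9 = r9) (h_r10 : u.reg .r10 = r10) (h_r11 : u.reg .r11 = r11) (h_r12 : u.reg .r12 = r12) (h_r13 : u.reg .r13 = r13) (h_r14 : u.reg .r14 = r14) (h_r15 : u.reg .r15 = r15) (h_rip : u.rip = 0x100000) (h_fl : u.flags = fl) (hμ : μ.vendor = .intel)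
    (hHas : ∀ a n, L.Has a n) (hCan : ∀ a : Word, a < 0x40000000)
    (hNF : ∀ {α : Type} (x : Option α), x ≠ none) (hfam : μ.cfg.field Feature.familyId = 6) (hQ : ∀ v, Q v) :
    InsnGoal L μ u Q (insn% [0x48, 0x01, 0xd8]) := by
  u_insn [h_rax, h_rcx, h_rdx, h_rbx, h_rsp, h_rbp, h_rsi, h_rdi, h_r8, h_r9, h_r10, h_r11, h_r12, h_r13, h_r14, h_r15, h_rip, h_fl, hμ]
  all_goals first | exact hHas _ _ | exact hCan _ | exact hNF _ hopt1 | exact Or.inl hfam | exact hQ _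

/-- `add eax, dword ptr [rsp+0x4]` -/
example (h_rax : u.reg .rax = rax) (h_rcx : u.reg .rcx = rcx) (h_rdx : u.reg .rdx = rdx) (h_rbx : u.reg .rbx = rbx) (h_rsp : u.reg .rsp = rsp) (h_rbp : u.reg .rbp = rbp) (h_rsi : u.reg .rsi = rsi) (h_rdi : u.reg .rdi = rdi) (h_r8 : u.reg .r8 = r8) (h_r9 : u.reg .r9 = r9) (h_r10 : u.reg .r10 = r10) (h_r11 : u.reg .r11 = r11) (h_r12 : u.reg .r12 = r12) (h_r13 : u.reg .r13 = r13) (h_r14 : u.reg .r14 = r14) (h_r15 : u.reg .r15 = r15) (h_rip : u.rip = 0x100000) (h_fl : u.flags = fl) (hμ : μ.vendor = .intel)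
    (hHas : ∀ a n, L.Has a n) (hCan : ∀ a : Word, a < 0x40000000)
    (hNF : ∀ {α : Type} (x : Option α), x ≠ none) (hfam : μ.cfg.field Feature.familyId = 6) (hQ : ∀ v, Q v) :
    InsnGoal L μ u Q (insn% [0x03, 0x44, 0x24, 0x04]) := by
  u_insn [h_rax, h_rcx, h_rdx, h_rbx, h_rsp, h_rbp, h_rsi, h_rdi, h_r8, h_r9, h_r10, h_r11, h_r12, h_r13, h_r14, h_r15, h_rip, h_fl, hμ]
  all_goals first | exact hHas _ _ | exact hCan _ | exact hNF _ hopt1 | exact Or.inl hfam | exact hQ _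

/-- `add dword ptr [rbx+0x10], eax` -/
example (h_rax : u.reg .rax = rax) (h_rcx : u.reg .rcx = rcx) (h_rdx : u.reg .rdx = rdx) (h_rbx : u.reg .rbx = rbx) (h_rsp : u.reg .rsp = rsp) (h_rbp : u.reg .rbp = rbp) (h_rsi : u.reg .rsi = rsi) (h_rdi : u.reg .rdi = rdi) (h_r8 : u.reg .r8 = r8) (h_r9 : u.reg .r9 = r9) (h_r10 : u.reg .r10 = r10) (h_r11 : u.reg .r11 = r11) (h_r12 : u.reg .r12 = r12) (h_r13 : u.reg .r13 = r13) (h_r14 : u.reg .r14 = r14) (h_r15 : u.reg .r15 = r15) (h_rip : u.rip = 0x100000) (h_fl : u.flags = fl) (hμ : μ.vendor = .intel)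
    (hHas : ∀ a n, L.Has a n) (hCan : ∀ a : Word, a < 0x40000000)
    (hNF : ∀ {α : Type} (x : Option α), x ≠ none) (hfam : μ.cfg.field Feature.familyId = 6) (hQ : ∀ v, Q v) :
    InsnGoal L μ u Q (insn% [0x01, 0x43, 0x10]) := by
  u_insn [h_rax, h_rcx, h_rdx, h_rbx, h_rsp, h_rbp, h_rsi, h_rdi, h_r8, h_r9, h_r10, h_r11, h_r12, h_r13, h_r14, h_r15, h_rip, h_fl, hμ]
  all_goals first | exact hHas _ _ | exact hCan _ | exact hNF _ hopt1 | exact Or.inl hfam | exact hQ _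

/-- `add dword ptr [rbx+0x10], 0x1` -/
example (h_rax : u.reg .rax = rax) (h_rcx : u.reg .rcx = rcx) (h_rdx : u.reg .rdx = rdx) (h_rbx : u.reg .rbx = rbx) (h_rsp : u.reg .rsp = rsp) (h_rbp : u.reg .rbp = rbp) (h_rsi : u.reg .rsi = rsi) (h_rdi : u.reg .rdi = rdi) (h_r8 : u.reg .r8 = r8) (h_r9 : u.reg .r9 = r9) (h_r10 : u.reg .r10 = r10) (h_r11 : u.reg .r11 = r11) (h_r12 : u.reg .r12 = r12) (h_r13 : u.reg .r13 = r13) (h_r14 : u.reg .r14 = r14) (h_r15 : u.reg .r15 = r15) (h_rip : u.rip = 0x100000) (h_fl : u.flags = fl) (hμ : μ.vendor = .intel)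
    (hHas : ∀ a n, L.Has a n) (hCan : ∀ a : Word, a < 0x40000000)
    (hNF : ∀ {α : Type} (x : Option α), x ≠ none) (hfam : μ.cfg.field Feature.familyId = 6) (hQ : ∀ v, Q v) :
    InsnGoal L μ u Q (insn% [0x83, 0x43, 0x10, 0x01]) := by
  u_insn [h_rax, h_rcx, h_rdx, h_rbx, h_rsp, h_rbp, h_rsi, h_rdi, h_r8, h_r9, h_r10, h_r11, h_r12, h_r13, h_r14, h_r15, h_rip, h_fl, hμ]
  all_goals first | exact hHas _ _ | exact hCan _ | exact hNF _ hopt1 | exact Or.inl hfam | exact hQ _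

/-- `sub rsp, 0x18` -/
example (h_rax : u.reg .rax = rax) (h_rcx : u.reg .rcx = rcx) (h_rdx : u.reg .rdx = rdx) (h_rbx : u.reg .rbx = rbx) (h_rsp : u.reg .rsp = rsp) (h_rbp : u.reg .rbp = rbp) (h_rsi : u.reg .rsi = rsi) (h_rdi : u.reg .rdi = rdi) (h_r8 : u.reg .r8 = r8) (h_r9 : u.reg .r9 = r9) (h_r10 : u.reg .r10 = r10) (h_r11 : u.reg .r11 = r11) (h_r12 : u.reg .r12 = r12) (h_r13 : u.reg .r13 = r13) (h_r14 : u.reg .r14 = r14) (h_r15 : u.reg .r15 = r15) (h_rip : u.rip = 0x100000) (h_fl : u.flags = fl) (hμ : μ.vendor = .intel)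
    (hHas : ∀ a n, L.Has a n) (hCan : ∀ a : Word, a < 0x40000000)
    (hNF : ∀ {α : Type} (x : Option α), x ≠ none) (hfam : μ.cfg.field Feature.familyId = 6) (hQ : ∀ v, Q v) :
    InsnGoal L μ u Q (insn% [0x48, 0x83, 0xec, 0x18]) := by
  u_insn [h_rax, h_rcx, h_rdx, h_rbx, h_rsp, h_rbp, h_rsi, h_rdi, h_r8, h_r9, h_r10, h_r11, h_r12, h_r13, h_r14, h_r15, h_rip, h_fl, hμ]
  all_goals first | exact hHas _ _ | exact hCan _ | exact hNF _ hopt1 | exact Or.inl hfam | exact hQ _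

/-- `sub eax, ebx` -/
example (h_rax : u.reg .rax = rax) (h_rcx : u.reg .rcx = rcx) (h_rdx : u.reg .rdx = rdx) (h_rbx : u.reg .rbx = rbx) (h_rsp : u.reg .rsp = rsp) (h_rbp : u.reg .rbp = rbp) (h_rsi : u.reg .rsi = rsi) (h_rdi : u.reg .rdi = rdi) (h_r8 : u.reg .r8 = r8) (h_r9 : u.reg .r9 = r9) (h_r10 : u.reg .r10 = r10) (h_r11 : u.reg .r11 = r11) (h_r12 : u.reg .r12 = r12) (h_r13 : u.reg .r13 = r13) (h_r14 : u.reg .r14 = r14) (h_r15 : u.reg .r15 = r15) (h_rip : u.rip = 0x100000) (h_fl : u.flags = fl) (hμ : μ.vendor = .intel)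
    (hHas : ∀ a n, L.Has a n) (hCan : ∀ a : Word, a < 0x40000000)
    (hNF : ∀ {α : Type} (x : Option α), x ≠ none) (hfam : μ.cfg.field Feature.familyId = 6) (hQ : ∀ v, Q v) :
    InsnGoal L μ u Q (insn% [0x29, 0xd8]) := by
  u_insn [h_rax, h_rcx, h_rdx, h_rbx, h_rsp, h_rbp, h_rsi, h_rdi, h_r8, h_r9, h_r10, h_r11, h_r12, h_r13, h_r14, h_r15, h_rip, h_fl, hμ]
  all_goals first | exact hHas _ _ | exact hCan _ | exact hNF _ hopt1 | exact Or.inl hfam | exact hQ _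

/-- `and eax, 0x7` -/
example (h_rax : u.reg .rax = rax) (h_rcx : u.reg .rcx = rcx) (h_rdx : u.reg .rdx = rdx) (h_rbx : u.reg .rbx = rbx) (h_rsp : u.reg .rsp = rsp) (h_rbp : u.reg .rbp = rbp) (h_rsi : u.reg .rsi = rsi) (h_rdi : u.reg .rdi = rdi) (h_r8 : u.reg .r8 = r8) (h_r9 : u.reg .r9 = r9) (h_r10 : u.reg .r10 = r10) (h_r11 : u.reg .r11 = r11) (h_r12 : u.reg .r12 = r12) (h_r13 : u.reg .r13 = r13) (h_r14 : u.reg .r14 = r14) (h_r15 : u.reg .r15 = r15) (h_rip : u.rip = 0x100000) (h_fl : u.flags = fl) (hμ : μ.vendor = .intel)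
    (hHas : ∀ a n, L.Has a n) (hCan : ∀ a : Word, a < 0x40000000)
    (hNF : ∀ {α : Type} (x : Option α), x ≠ none) (hfam : μ.cfg.field Feature.familyId = 6) (hQ : ∀ v, Q v) :
    InsnGoal L μ u Q (insn% [0x83, 0xe0, 0x07]) := by
  u_insn [h_rax, h_rcx, h_rdx, h_rbx, h_rsp, h_rbp, h_rsi, h_rdi, h_r8, h_r9, h_r10, h_r11, h_r12, h_r13, h_r14, h_r15, h_rip, h_fl, hμ]
  all_goals first | exact hHas _ _ | exact hCan _ | exact hNF _ hopt1 | exact Or.inl hfam | exact hQ _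

/-- `and ebx, 0x3ff` -/
example (h_rax : u.reg .rax = rax) (h_rcx : u.reg .rcx = rcx) (h_rdx : u.reg .rdx = rdx) (h_rbx : u.reg .rbx = rbx) (h_rsp : u.reg .rsp = rsp) (h_rbp : u.reg .rbp = rbp) (h_rsi : u.reg .rsi = rsi) (h_rdi : u.reg .rdi = rdi) (h_r8 : u.reg .r8 = r8) (h_r9 : u.reg .r9 = r9) (h_r10 : u.reg .r10 = r10) (h_r11 : u.reg .r11 = r11) (h_r12 : u.reg .r12 = r12) (h_r13 : u.reg .r13 = r13) (h_r14 : u.reg .r14 = r14) (h_r15 : u.reg .r15 = r15) (h_rip : u.rip = 0x100000) (h_fl : u.flags = fl) (hμ : μ.vendor = .intel)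
    (hHas : ∀ a n, L.Has a n) (hCan : ∀ a : Word, a < 0x40000000)
    (hNF : ∀ {α : Type} (x : Option α), x ≠ none) (hfam : μ.cfg.field Feature.familyId = 6) (hQ : ∀ v, Q v) :
    InsnGoal L μ u Q (insn% [0x81, 0xe3, 0xff, 0x03, 0x00, 0x00]) := by
  u_insn [h_rax, h_rcx, h_rdx, h_rbx, h_rsp, h_rbp, h_rsi, h_rdi, h_r8, h_r9, h_r10, h_r11, h_r12, h_r13, h_r14, h_r15, h_rip, h_fl, hμ]
  all_goals first | exact hHas _ _ | exact hCan _ | exact hNF _ hopt1 | exact Or.inl hfam | exact hQ _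

/-- `or rdx, rsi` -/
example (h_rax : u.reg .rax = rax) (h_rcx : u.reg .rcx = rcx) (h_rdx : u.reg .rdx = rdx) (h_rbx : u.reg .rbx = rbx) (h_rsp : u.reg .rsp = rsp) (h_rbp : u.reg .rbp = rbp) (h_rsi : u.reg .rsi = rsi) (h_rdi : u.reg .rdi = rdi) (h_r8 : u.reg .r8 = r8) (h_r9 : u.reg .r9 = r9) (h_r10 : u.reg .r10 = r10) (h_r11 : u.reg .r11 = r11) (h_r12 : u.reg .r12 = r12) (h_r13 : u.reg .r13 = r13) (h_r14 : u.reg .r14 = r14) (h_r15 : u.reg .r15 = r15) (h_rip : u.rip = 0x100000) (h_fl : u.flags = fl) (hμ : μ.vendor = .intel)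
    (hHas : ∀ a n, L.Has a n) (hCan : ∀ a : Word, a < 0x40000000)
    (hNF : ∀ {α : Type} (x : Option α), x ≠ none) (hfam : μ.cfg.field Feature.familyId = 6) (hQ : ∀ v, Q v) :
    InsnGoal L μ u Q (insn% [0x48, 0x09, 0xf2]) := by
  u_insn [h_rax, h_rcx, h_rdx, h_rbx, h_rsp, h_rbp, h_rsi, h_rdi, h_r8, h_r9, h_r10, h_r11, h_r12, h_r13, h_r14, h_r15, h_rip, h_fl, hμ]
  all_goals first | exact hHas _ _ | exact hCan _ | exact hNF _ hopt1 | exact Or.inl hfam | exact hQ _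

/-- `xor ebx, edx` -/
example (h_rax : u.reg .rax = rax) (h_rcx : u.reg .rcx = rcx) (h_rdx : u.reg .rdx = rdx) (h_rbx : u.reg .rbx = rbx) (h_rsp : u.reg .rsp = rsp) (h_rbp : u.reg .rbp = rbp) (h_rsi : u.reg .rsi = rsi) (h_rdi : u.reg .rdi = rdi) (h_r8 : u.reg .r8 = r8) (h_r9 : u.reg .r9 = r9) (h_r10 : u.reg .r10 = r10) (h_r11 : u.reg .r11 = r11) (h_r12 : u.reg .r12 = r12) (h_r13 : u.reg .r13 = r13) (h_r14 : u.reg .r14 = r14) (h_r15 : u.reg .r15 = r15) (h_rip : u.rip = 0x100000) (h_fl : u.flags = fl) (hμ : μ.vendor = .intel)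
    (hHas : ∀ a n, L.Has a n) (hCan : ∀ a : Word, a < 0x40000000)
    (hNF : ∀ {α : Type} (x : Option α), x ≠ none) (hfam : μ.cfg.field Feature.familyId = 6) (hQ : ∀ v, Q v) :
    InsnGoal L μ u Q (insn% [0x31, 0xd3]) := by
  u_insn [h_rax, h_rcx, h_rdx, h_rbx, h_rsp, h_rbp, h_rsi, h_rdi, h_r8, h_r9, h_r10, h_r11, h_r12, h_r13, h_r14, h_r15, h_rip, h_fl, hμ]
  all_goals first | exact hHas _ _ | exact hCan _ | exact hNF _ hopt1 | exact Or.inl hfam | exact hQ _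

/-- `xor eax, eax` -/
example (h_rax : u.reg .rax = rax) (h_rcx : u.reg .rcx = rcx) (h_rdx : u.reg .rdx = rdx) (h_rbx : u.reg .rbx = rbx) (h_rsp : u.reg .rsp = rsp) (h_rbp : u.reg .rbp = rbp) (h_rsi : u.reg .rsi = rsi) (h_rdi : u.reg .rdi = rdi) (h_r8 : u.reg .r8 = r8) (h_r9 : u.reg .r9 = r9) (h_r10 : u.reg .r10 = r10) (h_r11 : u.reg .r11 = r11) (h_r12 : u.reg .r12 = r12) (h_r13 : u.reg .r13 = r13) (h_r14 : u.reg .r14 = r14) (h_r15 : u.reg .r15 = r15) (h_rip : u.rip = 0x100000) (h_fl : u.flags = fl) (hμ : μ.vendor = .intel)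
    (hHas : ∀ a n, L.Has a n) (hCan : ∀ a : Word, a < 0x40000000)
    (hNF : ∀ {α : Type} (x : Option α), x ≠ none) (hfam : μ.cfg.field Feature.familyId = 6) (hQ : ∀ v, Q v) :
    InsnGoal L μ u Q (insn% [0x31, 0xc0]) := by
  u_insn [h_rax, h_rcx, h_rdx, h_rbx, h_rsp, h_rbp, h_rsi, h_rdi, h_r8, h_r9, h_r10, h_r11, h_r12, h_r13, h_r14, h_r15, h_rip, h_fl, hμ]
  all_goals first | exact hHas _ _ | exact hCan _ | exact hNF _ hopt1 | exact Or.inl hfam | exact hQ _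

/-- `cmp rdi, 0xffffef` -/
example (h_rax : u.reg .rax = rax) (h_rcx : u.reg .rcx = rcx) (h_rdx : u.reg .rdx = rdx) (h_rbx : u.reg .rbx = rbx) (h_rsp : u.reg .rsp = rsp) (h_rbp : u.reg .rbp = rbp) (h_rsi : u.reg .rsi = rsi) (h_rdi : u.reg .rdi = rdi) (h_r8 : u.reg .r8 = r8) (h_r9 : u.reg .r9 = r9) (h_r10 : u.reg .r10 = r10) (h_r11 : u.reg .r11 = r11) (h_r12 : u.reg .r12 = r12) (h_r13 : u.reg .r13 = r13) (h_r14 : u.reg .r14 = r14) (h_r15 : u.reg .r15 = r15) (h_rip : u.rip = 0x100000) (h_fl : u.flags = fl) (hμ : μ.vendor = .intel)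
    (hHas : ∀ a n, L.Has a n) (hCan : ∀ a : Word, a < 0x40000000)
    (hNF : ∀ {α : Type} (x : Option α), x ≠ none) (hfam : μ.cfg.field Feature.familyId = 6) (hQ : ∀ v, Q v) :
    InsnGoal L μ u Q (insn% [0x48, 0x81, 0xff, 0xef, 0xff, 0xff, 0x00]) := by
  u_insn [h_rax, h_rcx, h_rdx, h_rbx, h_rsp, h_rbp, h_rsi, h_rdi, h_r8, h_r9, h_r10, h_r11, h_r12, h_r13, h_r14, h_r15, h_rip, h_fl, hμ]
  all_goals first | exact hHas _ _ | exact hCan _ | exact hNF _ hopt1 | exact Or.inl hfam | exact hQ _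

/-- `cmp eax, ebp` -/
example (h_rax : u.reg .rax = rax) (h_rcx : u.reg .rcx = rcx) (h_rdx : u.reg .rdx = rdx) (h_rbx : u.reg .rbx = rbx) (h_rsp : u.reg .rsp = rsp) (h_rbp : u.reg .rbp = rbp) (h_rsi : u.reg .rsi = rsi) (h_rdi : u.reg .rdi = rdi) (h_r8 : u.reg .r8 = r8) (h_r9 : u.reg .r9 = r9) (h_r10 : u.reg .r10 = r10) (h_r11 : u.reg .r11 = r11) (h_r12 : u.reg .r12 = r12) (h_r13 : u.reg .r13 = r13) (h_r14 : u.reg .r14 = r14) (h_r15 : u.reg .r15 = r15) (h_rip : u.rip = 0x100000) (h_fl : u.flags = fl) (hμ : μ.vendor = .intel)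
    (hHas : ∀ a n, L.Has a n) (hCan : ∀ a : Word, a < 0x40000000)
    (hNF : ∀ {α : Type} (x : Option α), x ≠ none) (hfam : μ.cfg.field Feature.familyId = 6) (hQ : ∀ v, Q v) :
    InsnGoal L μ u Q (insn% [0x39, 0xe8]) := by
  u_insn [h_rax, h_rcx, h_rdx, h_rbx, h_rsp, h_rbp, h_rsi, h_rdi, h_r8, h_r9, h_r10, h_r11, h_r12, h_r13, h_r14, h_r15, h_rip, h_fl, hμ]
  all_goals first | exact hHas _ _ | exact hCan _ | exact hNF _ hopt1 | exact Or.inl hfam | exact hQ _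

/-- `cmp eax, -1` -/
example (h_rax : u.reg .rax = rax) (h_rcx : u.reg .rcx = rcx) (h_rdx : u.reg .rdx = rdx) (h_rbx : u.reg .rbx = rbx) (h_rsp : u.reg .rsp = rsp) (h_rbp : u.reg .rbp = rbp) (h_rsi : u.reg .rsi = rsi) (h_rdi : u.reg .rdi = rdi) (h_r8 : u.reg .r8 = r8) (h_r9 : u.reg .r9 = r9) (h_r10 : u.reg .r10 = r10) (h_r11 : u.reg .r11 = r11) (h_r12 : u.reg .r12 = r12) (h_r13 : u.reg .r13 = r13) (h_r14 : u.reg .r14 = r14) (h_r15 : u.reg .r15 = r15) (h_rip : u.rip = 0x100000) (h_fl : u.flags = fl) (hμ : μ.vendor = .intel)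
    (hHas : ∀ a n, L.Has a n) (hCan : ∀ a : Word, a < 0x40000000)
    (hNF : ∀ {α : Type} (x : Option α), x ≠ none) (hfam : μ.cfg.field Feature.familyId = 6) (hQ : ∀ v, Q v) :
    InsnGoal L μ u Q (insn% [0x83, 0xf8, 0xff]) := by
  u_insn [h_rax, h_rcx, h_rdx, h_rbx, h_rsp, h_rbp, h_rsi, h_rdi, h_r8, h_r9, h_r10, h_r11, h_r12, h_r13, h_r14, h_r15, h_rip, h_fl, hμ]
  all_goals first | exact hHas _ _ | exact hCan _ | exact hNF _ hopt1 | exact Or.inl hfam | exact hQ _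

/-- `cmp byte ptr [rcx+0xc00000], 0x0` -/
example (h_rax : u.reg .rax = rax) (h_rcx : u.reg .rcx = rcx) (h_rdx : u.reg .rdx = rdx) (h_rbx : u.reg .rbx = rbx) (h_rsp : u.reg .rsp = rsp) (h_rbp : u.reg .rbp = rbp) (h_rsi : u.reg .rsi = rsi) (h_rdi : u.reg .rdi = rdi) (h_r8 : u.reg .r8 = r8) (h_r9 : u.reg .r9 = r9) (h_r10 : u.reg .r10 = r10) (h_r11 : u.reg .r11 = r11) (h_r12 : u.reg .r12 = r12) (h_r13 : u.reg .r13 = r13) (h_r14 : u.reg .r14 = r14) (h_r15 : u.reg .r15 = r15) (h_rip : u.rip = 0x100000) (h_fl : u.flags = fl) (hμ : μ.vendor = .intel)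
    (hHas : ∀ a n, L.Has a n) (hCan : ∀ a : Word, a < 0x40000000)
    (hNF : ∀ {α : Type} (x : Option α), x ≠ none) (hfam : μ.cfg.field Feature.familyId = 6) (hQ : ∀ v, Q v) :
    InsnGoal L μ u Q (insn% [0x80, 0xb9, 0x00, 0x00, 0xc0, 0x00, 0x00]) := by
  u_insn [h_rax, h_rcx, h_rdx, h_rbx, h_rsp, h_rbp, h_rsi, h_rdi, h_r8, h_r9, h_r10, h_r11, h_r12, h_r13, h_r14, h_r15, h_rip, h_fl, hμ]
  all_goals first | exact hHas _ _ | exact hCan _ | exact hNF _ hopt1 | exact Or.inl hfam | exact hQ _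

/-- `cmp dl, al` -/
example (h_rax : u.reg .rax = rax) (h_rcx : u.reg .rcx = rcx) (h_rdx : u.reg .rdx = rdx) (h_rbx : u.reg .rbx = rbx) (h_rsp : u.reg .rsp = rsp) (h_rbp : u.reg .rbp = rbp) (h_rsi : u.reg .rsi = rsi) (h_rdi : u.reg .rdi = rdi) (h_r8 : u.reg .r8 = r8) (h_r9 : u.reg .r9 = r9) (h_r10 : u.reg .r10 = r10) (h_r11 : u.reg .r11 = r11) (h_r12 : u.reg .r12 = r12) (h_r13 : u.reg .r13 = r13) (h_r14 : u.reg .r14 = r14) (h_r15 : u.reg .r15 = r15) (h_rip : u.rip = 0x100000) (h_fl : u.flags = fl) (hμ : μ.vendor = .intel)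
    (hHas : ∀ a n, L.Has a n) (hCan : ∀ a : Word, a < 0x40000000)
    (hNF : ∀ {α : Type} (x : Option α), x ≠ none) (hfam : μ.cfg.field Feature.familyId = 6) (hQ : ∀ v, Q v) :
    InsnGoal L μ u Q (insn% [0x38, 0xc2]) := by
  u_insn [h_rax, h_rcx, h_rdx, h_rbx, h_rsp, h_rbp, h_rsi, h_rdi, h_r8, h_r9, h_r10, h_r11, h_r12, h_r13, h_r14, h_r15, h_rip, h_fl, hμ]
  all_goals first | exact hHas _ _ | exact hCan _ | exact hNF _ hopt1 | exact Or.inl hfam | exact hQ _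

/-- `test eax, eax` -/
example (h_rax : u.reg .rax = rax) (h_rcx : u.reg .rcx = rcx) (h_rdx : u.reg .rdx = rdx) (h_rbx : u.reg .rbx = rbx) (h_rsp : u.reg .rsp = rsp) (h_rbp : u.reg .rbp = rbp) (h_rsi : u.reg .rsi = rsi) (h_rdi : u.reg .rdi = rdi) (h_r8 : u.reg .r8 = r8) (h_r9 : u.reg .r9 = r9) (h_r10 : u.reg .r10 = r10) (h_r11 : u.reg .r11 = r11) (h_r12 : u.reg .r12 = r12) (h_r13 : u.reg .r13 = r13) (h_r14 : u.reg .r14 = r14) (h_r15 : u.reg .r15 = r15) (h_rip : u.rip = 0x100000) (h_fl : u.flags = fl) (hμ : μ.vendor = .intel)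
    (hHas : ∀ a n, L.Has a n) (hCan : ∀ a : Word, a < 0x40000000)
    (hNF : ∀ {α : Type} (x : Option α), x ≠ none) (hfam : μ.cfg.field Feature.familyId = 6) (hQ : ∀ v, Q v) :
    InsnGoal L μ u Q (insn% [0x85, 0xc0]) := by
  u_insn [h_rax, h_rcx, h_rdx, h_rbx, h_rsp, h_rbp, h_rsi, h_rdi, h_r8, h_r9, h_r10, h_r11, h_r12, h_r13, h_r14, h_r15, h_rip, h_fl, hμ]
  all_goals first | exact hHas _ _ | exact hCan _ | exact hNF _ hopt1 | exact Or.inl hfam | exact hQ _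

/-- `test al, al` -/
example (h_rax : u.reg .rax = rax) (h_rcx : u.reg .rcx = rcx) (h_rdx : u.reg .rdx = rdx) (h_rbx : u.reg .rbx = rbx) (h_rsp : u.reg .rsp = rsp) (h_rbp : u.reg .rbp = rbp) (h_rsi : u.reg .rsi = rsi) (h_rdi : u.reg .rdi = rdi) (h_r8 : u.reg .r8 = r8) (h_r9 : u.reg .r9 = r9) (h_r10 : u.reg .r10 = r10) (h_r11 : u.reg .r11 = r11) (h_r12 : u.reg .r12 = r12) (h_r13 : u.reg .r13 = r13) (h_r14 : u.reg .r14 = r14) (h_r15 : u.reg .r15 = r15) (h_rip : u.rip = 0x100000) (h_fl : u.flags = fl) (hμ : μ.vendor = .intel)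
    (hHas : ∀ a n, L.Has a n) (hCan : ∀ a : Word, a < 0x40000000)
    (hNF : ∀ {α : Type} (x : Option α), x ≠ none) (hfam : μ.cfg.field Feature.familyId = 6) (hQ : ∀ v, Q v) :
    InsnGoal L μ u Q (insn% [0x84, 0xc0]) := by
  u_insn [h_rax, h_rcx, h_rdx, h_rbx, h_rsp, h_rbp, h_rsi, h_rdi, h_r8, h_r9, h_r10, h_r11, h_r12, h_r13, h_r14, h_r15, h_rip, h_fl, hμ]
  all_goals first | exact hHas _ _ | exact hCan _ | exact hNF _ hopt1 | exact Or.inl hfam | exact hQ _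

/-- `test r13, r13` -/
example (h_rax : u.reg .rax = rax) (h_rcx : u.reg .rcx = rcx) (h_rdx : u.reg .rdx = rdx) (h_rbx : u.reg .rbx = rbx) (h_rsp : u.reg .rsp = rsp) (h_rbp : u.reg .rbp = rbp) (h_rsi : u.reg .rsi = rsi) (h_rdi : u.reg .rdi = rdi) (h_r8 : u.reg .r8 = r8) (h_r9 : u.reg .r9 = r9) (h_r10 : u.reg .r10 = r10) (h_r11 : u.reg .r11 = r11) (h_r12 : u.reg .r12 = r12) (h_r13 : u.reg .r13 = r13) (h_r14 : u.reg .r14 = r14) (h_r15 : u.reg .r15 = r15) (h_rip : u.rip = 0x100000) (h_fl : u.flags = fl) (hμ : μ.vendor = .intel)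
    (hHas : ∀ a n, L.Has a n) (hCan : ∀ a : Word, a < 0x40000000)
    (hNF : ∀ {α : Type} (x : Option α), x ≠ none) (hfam : μ.cfg.field Feature.familyId = 6) (hQ : ∀ v, Q v) :
    InsnGoal L μ u Q (insn% [0x4d, 0x85, 0xed]) := by
  u_insn [h_rax, h_rcx, h_rdx, h_rbx, h_rsp, h_rbp, h_rsi, h_rdi, h_r8, h_r9, h_r10, h_r11, h_r12, h_r13, h_r14, h_r15, h_rip, h_fl, hμ]
  all_goals first | exact hHas _ _ | exact hCan _ | exact hNF _ hopt1 | exact Or.inl hfam | exact hQ _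

/-- `inc ecx` -/
example (h_rax : u.reg .rax = rax) (h_rcx : u.reg .rcx = rcx) (h_rdx : u.reg .rdx = rdx) (h_rbx : u.reg .rbx = rbx) (h_rsp : u.reg .rsp = rsp) (h_rbp : u.reg .rbp = rbp) (h_rsi : u.reg .rsi = rsi) (h_rdi : u.reg .rdi = rdi) (h_r8 : u.reg .r8 = r8) (h_r9 : u.reg .r9 = r9) (h_r10 : u.reg .r10 = r10) (h_r11 : u.reg .r11 = r11) (h_r12 : u.reg .r12 = r12) (h_r13 : u.reg .r13 = r13) (h_r14 : u.reg .r14 = r14) (h_r15 : u.reg .r15 = r15) (h_rip : u.rip = 0x100000) (h_fl : u.flags = fl) (hμ : μ.vendor = .intel)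
    (hHas : ∀ a n, L.Has a n) (hCan : ∀ a : Word, a < 0x40000000)
    (hNF : ∀ {α : Type} (x : Option α), x ≠ none) (hfam : μ.cfg.field Feature.familyId = 6) (hQ : ∀ v, Q v) :
    InsnGoal L μ u Q (insn% [0xff, 0xc1]) := by
  u_insn [h_rax, h_rcx, h_rdx, h_rbx, h_rsp, h_rbp, h_rsi, h_rdi, h_r8, h_r9, h_r10, h_r11, h_r12, h_r13, h_r14, h_r15, h_rip, h_fl, hμ]
  all_goals first | exact hHas _ _ | exact hCan _ | exact hNF _ hopt1 | exact Or.inl hfam | exact hQ _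

/-- `dec rdx` -/
example (h_rax : u.reg .rax = rax) (h_rcx : u.reg .rcx = rcx) (h_rdx : u.reg .rdx = rdx) (h_rbx : u.reg .rbx = rbx) (h_rsp : u.reg .rsp = rsp) (h_rbp : u.reg .rbp = rbp) (h_rsi : u.reg .rsi = rsi) (h_rdi : u.reg .rdi = rdi) (h_r8 : u.reg .r8 = r8) (h_r9 : u.reg .r9 = r9) (h_r10 : u.reg .r10 = r10) (h_r11 : u.reg .r11 = r11) (h_r12 : u.reg .r12 = r12) (h_r13 : u.reg .r13 = r13) (h_r14 : u.reg .r14 = r14) (h_r15 : u.reg .r15 = r15) (h_rip : u.rip = 0x100000) (h_fl : u.flags = fl) (hμ : μ.vendor = .intel)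
    (hHas : ∀ a n, L.Has a n) (hCan : ∀ a : Word, a < 0x40000000)
    (hNF : ∀ {α : Type} (x : Option α), x ≠ none) (hfam : μ.cfg.field Feature.familyId = 6) (hQ : ∀ v, Q v) :
    InsnGoal L μ u Q (insn% [0x48, 0xff, 0xca]) := by
  u_insn [h_rax, h_rcx, h_rdx, h_rbx, h_rsp, h_rbp, h_rsi, h_rdi, h_r8, h_r9, h_r10, h_r11, h_r12, h_r13, h_r14, h_r15, h_rip, h_fl, hμ]
  all_goals first | exact hHas _ _ | exact hCan _ | exact hNF _ hopt1 | exact Or.inl hfam | exact hQ _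

/-- `inc dword ptr [rbx]` -/
example (h_rax : u.reg .rax = rax) (h_rcx : u.reg .rcx = rcx) (h_rdx : u.reg .rdx = rdx) (h_rbx : u.reg .rbx = rbx) (h_rsp : u.reg .rsp = rsp) (h_rbp : u.reg .rbp = rbp) (h_rsi : u.reg .rsi = rsi) (h_rdi : u.reg .rdi = rdi) (h_r8 : u.reg .r8 = r8) (h_r9 : u.reg .r9 = r9) (h_r10 : u.reg .r10 = r10) (h_r11 : u.reg .r11 = r11) (h_r12 : u.reg .r12 = r12) (h_r13 : u.reg .r13 = r13) (h_r14 : u.reg .r14 = r14) (h_r15 : u.reg .r15 = r15) (h_rip : u.rip = 0x100000) (h_fl : u.flags = fl) (hμ : μ.vendor = .intel)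
    (hHas : ∀ a n, L.Has a n) (hCan : ∀ a : Word, a < 0x40000000)
    (hNF : ∀ {α : Type} (x : Option α), x ≠ none) (hfam : μ.cfg.field Feature.familyId = 6) (hQ : ∀ v, Q v) :
    InsnGoal L μ u Q (insn% [0xff, 0x03]) := by
  u_insn [h_rax, h_rcx, h_rdx, h_rbx, h_rsp, h_rbp, h_rsi, h_rdi, h_r8, h_r9, h_r10, h_r11, h_r12, h_r13, h_r14, h_r15, h_rip, h_fl, hμ]
  all_goals first | exact hHas _ _ | exact hCan _ | exact hNF _ hopt1 | exact Or.inl hfam | exact hQ _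

/-- `neg ebx` -/
example (h_rax : u.reg .rax = rax) (h_rcx : u.reg .rcx = rcx) (h_rdx : u.reg .rdx = rdx) (h_rbx : u.reg .rbx = rbx) (h_rsp : u.reg .rsp = rsp) (h_rbp : u.reg .rbp = rbp) (h_rsi : u.reg .rsi = rsi) (h_rdi : u.reg .rdi = rdi) (h_r8 : u.reg .r8 = r8) (h_r9 : u.reg .r9 = r9) (h_r10 : u.reg .r10 = r10) (h_r11 : u.reg .r11 = r11) (h_r12 : u.reg .r12 = r12) (h_r13 : u.reg .r13 = r13) (h_r14 : u.reg .r14 = r14) (h_r15 : u.reg .r15 = r15) (h_rip : u.rip = 0x100000) (h_fl : u.flags = fl) (hμ : μ.vendor = .intel)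
    (hHas : ∀ a n, L.Has a n) (hCan : ∀ a : Word, a < 0x40000000)
    (hNF : ∀ {α : Type} (x : Option α), x ≠ none) (hfam : μ.cfg.field Feature.familyId = 6) (hQ : ∀ v, Q v) :
    InsnGoal L μ u Q (insn% [0xf7, 0xdb]) := by
  u_insn [h_rax, h_rcx, h_rdx, h_rbx, h_rsp, h_rbp, h_rsi, h_rdi, h_r8, h_r9, h_r10, h_r11, h_r12, h_r13, h_r14, h_r15, h_rip, h_fl, hμ]
  all_goals first | exact hHas _ _ | exact hCan _ | exact hNF _ hopt1 | exact Or.inl hfam | exact hQ _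

/-- `not rdx` -/
example (h_rax : u.reg .rax = rax) (h_rcx : u.reg .rcx = rcx) (h_rdx : u.reg .rdx = rdx) (h_rbx : u.reg .rbx = rbx) (h_rsp : u.reg .rsp = rsp) (h_rbp : u.reg .rbp = rbp) (h_rsi : u.reg .rsi = rsi) (h_rdi : u.reg .rdi = rdi) (h_r8 : u.reg .r8 = r8) (h_r9 : u.reg .r9 = r9) (h_r10 : u.reg .r10 = r10) (h_r11 : u.reg .r11 = r11) (h_r12 : u.reg .r12 = r12) (h_r13 : u.reg .r13 = r13) (h_r14 : u.reg .r14 = r14) (h_r15 : u.reg .r15 = r15) (h_rip : u.rip = 0x100000) (h_fl : u.flags = fl) (hμ : μ.vendor = .intel)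
    (hHas : ∀ a n, L.Has a n) (hCan : ∀ a : Word, a < 0x40000000)
    (hNF : ∀ {α : Type} (x : Option α), x ≠ none) (hfam : μ.cfg.field Feature.familyId = 6) (hQ : ∀ v, Q v) :
    InsnGoal L μ u Q (insn% [0x48, 0xf7, 0xd2]) := by
  u_insn [h_rax, h_rcx, h_rdx, h_rbx, h_rsp, h_rbp, h_rsi, h_rdi, h_r8, h_r9, h_r10, h_r11, h_r12, h_r13, h_r14, h_r15, h_rip, h_fl, hμ]
  all_goals first | exact hHas _ _ | exact hCan _ | exact hNF _ hopt1 | exact Or.inl hfam | exact hQ _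

/-- `imul rax, rax, 0x848` -/
example (h_rax : u.reg .rax = rax) (h_rcx : u.reg .rcx = rcx) (h_rdx : u.reg .rdx = rdx) (h_rbx : u.reg .rbx = rbx) (h_rsp : u.reg .rsp = rsp) (h_rbp : u.reg .rbp = rbp) (h_rsi : u.reg .rsi = rsi) (h_rdi : u.reg .rdi = rdi) (h_r8 : u.reg .r8 = r8) (h_r9 : u.reg .r9 = r9) (h_r10 : u.reg .r10 = r10) (h_r11 : u.reg .r11 = r11) (h_r12 : u.reg .r12 = r12) (h_r13 : u.reg .r13 = r13) (h_r14 : u.reg .r14 = r14) (h_r15 : u.reg .r15 = r15) (h_rip : u.rip = 0x100000) (h_fl : u.flags = fl) (hμ : μ.vendor = .intel)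
    (hHas : ∀ a n, L.Has a n) (hCan : ∀ a : Word, a < 0x40000000)
    (hNF : ∀ {α : Type} (x : Option α), x ≠ none) (hfam : μ.cfg.field Feature.familyId = 6) (hQ : ∀ v, Q v) :
    InsnGoal L μ u Q (insn% [0x48, 0x69, 0xc0, 0x48, 0x08, 0x00, 0x00]) := by
  u_insn [h_rax, h_rcx, h_rdx, h_rbx, h_rsp, h_rbp, h_rsi, h_rdi, h_r8, h_r9, h_r10, h_r11, h_r12, h_r13, h_r14, h_r15, h_rip, h_fl, hμ]
  all_goals first | exact hHas _ _ | exact hCan _ | exact hNF _ hopt1 | exact Or.inl hfam | exact hQ _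

/-- `imul r12, r12, 0x3` -/
example (h_rax : u.reg .rax = rax) (h_rcx : u.reg .rcx = rcx) (h_rdx : u.reg .rdx = rdx) (h_rbx : u.reg .rbx = rbx) (h_rsp : u.reg .rsp = rsp) (h_rbp : u.reg .rbp = rbp) (h_rsi : u.reg .rsi = rsi) (h_rdi : u.reg .rdi = rdi) (h_r8 : u.reg .r8 = r8) (h_r9 : u.reg .r9 = r9) (h_r10 : u.reg .r10 = r10) (h_r11 : u.reg .r11 = r11) (h_r12 : u.reg .r12 = r12) (h_r13 : u.reg .r13 = r13) (h_r14 : u.reg .r14 = r14) (h_r15 : u.reg .r15 = r15) (h_rip : u.rip = 0x100000) (h_fl : u.flags = fl) (hμ : μ.vendor = .intel)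
    (hHas : ∀ a n, L.Has a n) (hCan : ∀ a : Word, a < 0x40000000)
    (hNF : ∀ {α : Type} (x : Option α), x ≠ none) (hfam : μ.cfg.field Feature.familyId = 6) (hQ : ∀ v, Q v) :
    InsnGoal L μ u Q (insn% [0x4d, 0x6b, 0xe4, 0x03]) := by
  u_insn [h_rax, h_rcx, h_rdx, h_rbx, h_rsp, h_rbp, h_rsi, h_rdi, h_r8, h_r9, h_r10, h_r11, h_r12, h_r13, h_r14, h_r15, h_rip, h_fl, hμ]
  all_goals first | exact hHas _ _ | exact hCan _ | exact hNF _ hopt1 | exact Or.inl hfam | exact hQ _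

/-- `imul eax, r15d` -/
example (h_rax : u.reg .rax = rax) (h_rcx : u.reg .rcx = rcx) (h_rdx : u.reg .rdx = rdx) (h_rbx : u.reg .rbx = rbx) (h_rsp : u.reg .rsp = rsp) (h_rbp : u.reg .rbp = rbp) (h_rsi : u.reg .rsi = rsi) (h_rdi : u.reg .rdi = rdi) (h_r8 : u.reg .r8 = r8) (h_r9 : u.reg .r9 = r9) (h_r10 : u.reg .r10 = r10) (h_r11 : u.reg .r11 = r11) (h_r12 : u.reg .r12 = r12) (h_r13 : u.reg .r13 = r13) (h_r14 : u.reg .r14 = r14) (h_r15 : u.reg .r15 = r15) (h_rip : u.rip = 0x100000) (h_fl : u.flags = fl) (hμ : μ.vendor = .intel)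
    (hHas : ∀ a n, L.Has a n) (hCan : ∀ a : Word, a < 0x40000000)
    (hNF : ∀ {α : Type} (x : Option α), x ≠ none) (hfam : μ.cfg.field Feature.familyId = 6) (hQ : ∀ v, Q v) :
    InsnGoal L μ u Q (insn% [0x41, 0x0f, 0xaf, 0xc7]) := by
  u_insn [h_rax, h_rcx, h_rdx, h_rbx, h_rsp, h_rbp, h_rsi, h_rdi, h_r8, h_r9, h_r10, h_r11, h_r12, h_r13, h_r14, h_r15, h_rip, h_fl, hμ]
  all_goals first | exact hHas _ _ | exact hCan _ | exact hNF _ hopt1 | exact Or.inl hfam | exact hQ _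

/-- `mul ebx` -/
example (h_rax : u.reg .rax = rax) (h_rcx : u.reg .rcx = rcx) (h_rdx : u.reg .rdx = rdx) (h_rbx : u.reg .rbx = rbx) (h_rsp : u.reg .rsp = rsp) (h_rbp : u.reg .rbp = rbp) (h_rsi : u.reg .rsi = rsi) (h_rdi : u.reg .rdi = rdi) (h_r8 : u.reg .r8 = r8) (h_r9 : u.reg .r9 = r9) (h_r10 : u.reg .r10 = r10) (h_r11 : u.reg .r11 = r11) (h_r12 : u.reg .r12 = r12) (h_r13 : u.reg .r13 = r13) (h_r14 : u.reg .r14 = r14) (h_r15 : u.reg .r15 = r15) (h_rip : u.rip = 0x100000) (h_fl : u.flags = fl) (hμ : μ.vendor = .intel)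
    (hHas : ∀ a n, L.Has a n) (hCan : ∀ a : Word, a < 0x40000000)
    (hNF : ∀ {α : Type} (x : Option α), x ≠ none) (hfam : μ.cfg.field Feature.familyId = 6) (hQ : ∀ v, Q v) :
    InsnGoal L μ u Q (insn% [0xf7, 0xe3]) := by
  u_insn [h_rax, h_rcx, h_rdx, h_rbx, h_rsp, h_rbp, h_rsi, h_rdi, h_r8, h_r9, h_r10, h_r11, h_r12, h_r13, h_r14, h_r15, h_rip, h_fl, hμ]
  all_goals first | exact hHas _ _ | exact hCan _ | exact hNF _ hopt1 | exact Or.inl hfam | exact hQ _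

/-- `shl rbp, 0x2` -/
example (h_rax : u.reg .rax = rax) (h_rcx : u.reg .rcx = rcx) (h_rdx : u.reg .rdx = rdx) (h_rbx : u.reg .rbx = rbx) (h_rsp : u.reg .rsp = rsp) (h_rbp : u.reg .rbp = rbp) (h_rsi : u.reg .rsi = rsi) (h_rdi : u.reg .rdi = rdi) (h_r8 : u.reg .r8 = r8) (h_r9 : u.reg .r9 = r9) (h_r10 : u.reg .r10 = r10) (h_r11 : u.reg .r11 = r11) (h_r12 : u.reg .r12 = r12) (h_r13 : u.reg .r13 = r13) (h_r14 : u.reg .r14 = r14) (h_r15 : u.reg .r15 = r15) (h_rip : u.rip = 0x100000) (h_fl : u.flags = fl) (hμ : μ.vendor = .intel)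
    (hHas : ∀ a n, L.Has a n) (hCan : ∀ a : Word, a < 0x40000000)
    (hNF : ∀ {α : Type} (x : Option α), x ≠ none) (hfam : μ.cfg.field Feature.familyId = 6) (hQ : ∀ v, Q v) :
    InsnGoal L μ u Q (insn% [0x48, 0xc1, 0xe5, 0x02]) := by
  u_insn [h_rax, h_rcx, h_rdx, h_rbx, h_rsp, h_rbp, h_rsi, h_rdi, h_r8, h_r9, h_r10, h_r11, h_r12, h_r13, h_r14, h_r15, h_rip, h_fl, hμ]
  all_goals first | exact hHas _ _ | exact hCan _ | exact hNF _ hopt1 | exact Or.inl hfam | exact hQ _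

/-- `shl eax, cl` -/
example (h_rax : u.reg .rax = rax) (h_rcx : u.reg .rcx = rcx) (h_rdx : u.reg .rdx = rdx) (h_rbx : u.reg .rbx = rbx) (h_rsp : u.reg .rsp = rsp) (h_rbp : u.reg .rbp = rbp) (h_rsi : u.reg .rsi = rsi) (h_rdi : u.reg .rdi = rdi) (h_r8 : u.reg .r8 = r8) (h_r9 : u.reg .r9 = r9) (h_r10 : u.reg .r10 = r10) (h_r11 : u.reg .r11 = r11) (h_r12 : u.reg .r12 = r12) (h_r13 : u.reg .r13 = r13) (h_r14 : u.reg .r14 = r14) (h_r15 : u.reg .r15 = r15) (h_rip : u.rip = 0x100000) (h_fl : u.flags = fl) (hμ : μ.vendor = .intel)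
    (hHas : ∀ a n, L.Has a n) (hCan : ∀ a : Word, a < 0x40000000)
    (hNF : ∀ {α : Type} (x : Option α), x ≠ none) (hfam : μ.cfg.field Feature.familyId = 6) (hQ : ∀ v, Q v) :
    InsnGoal L μ u Q (insn% [0xd3, 0xe0]) := by
  u_insn [h_rax, h_rcx, h_rdx, h_rbx, h_rsp, h_rbp, h_rsi, h_rdi, h_r8, h_r9, h_r10, h_r11, h_r12, h_r13, h_r14, h_r15, h_rip, h_fl, hμ]
  all_goals first | exact hHas _ _ | exact hCan _ | exact hNF _ hopt1 | exact Or.inl hfam | exact hQ _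

/-- `shl eax, 1` -/
example (h_rax : u.reg .rax = rax) (h_rcx : u.reg .rcx = rcx) (h_rdx : u.reg .rdx = rdx) (h_rbx : u.reg .rbx = rbx) (h_rsp : u.reg .rsp = rsp) (h_rbp : u.reg .rbp = rbp) (h_rsi : u.reg .rsi = rsi) (h_rdi : u.reg .rdi = rdi) (h_r8 : u.reg .r8 = r8) (h_r9 : u.reg .r9 = r9) (h_r10 : u.reg .r10 = r10) (h_r11 : u.reg .r11 = r11) (h_r12 : u.reg .r12 = r12) (h_r13 : u.reg .r13 = r13) (h_r14 : u.reg .r14 = r14) (h_r15 : u.reg .r15 = r15) (h_rip : u.rip = 0x100000) (h_fl : u.flags = fl) (hμ : μ.vendor = .intel)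
    (hHas : ∀ a n, L.Has a n) (hCan : ∀ a : Word, a < 0x40000000)
    (hNF : ∀ {α : Type} (x : Option α), x ≠ none) (hfam : μ.cfg.field Feature.familyId = 6) (hQ : ∀ v, Q v) :
    InsnGoal L μ u Q (insn% [0xd1, 0xe0]) := by
  u_insn [h_rax, h_rcx, h_rdx, h_rbx, h_rsp, h_rbp, h_rsi, h_rdi, h_r8, h_r9, h_r10, h_r11, h_r12, h_r13, h_r14, h_r15, h_rip, h_fl, hμ]
  all_goals first | exact hHas _ _ | exact hCan _ | exact hNF _ hopt1 | exact Or.inl hfam | exact hQ _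

/-- `shr rdx, 0x3` -/
example (h_rax : u.reg .rax = rax) (h_rcx : u.reg .rcx = rcx) (h_rdx : u.reg .rdx = rdx) (h_rbx : u.reg .rbx = rbx) (h_rsp : u.reg .rsp = rsp) (h_rbp : u.reg .rbp = rbp) (h_rsi : u.reg .rsi = rsi) (h_rdi : u.reg .rdi = rdi) (h_r8 : u.reg .r8 = r8) (h_r9 : u.reg .r9 = r9) (h_r10 : u.reg .r10 = r10) (h_r11 : u.reg .r11 = r11) (h_r12 : u.reg .r12 = r12) (h_r13 : u.reg .r13 = r13) (h_r14 : u.reg .r14 = r14) (h_r15 : u.reg .r15 = r15) (h_rip : u.rip = 0x100000) (h_fl : u.flags = fl) (hμ : μ.vendor = .intel)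
    (hHas : ∀ a n, L.Has a n) (hCan : ∀ a : Word, a < 0x40000000)
    (hNF : ∀ {α : Type} (x : Option α), x ≠ none) (hfam : μ.cfg.field Feature.familyId = 6) (hQ : ∀ v, Q v) :
    InsnGoal L μ u Q (insn% [0x48, 0xc1, 0xea, 0x03]) := by
  u_insn [h_rax, h_rcx, h_rdx, h_rbx, h_rsp, h_rbp, h_rsi, h_rdi, h_r8, h_r9, h_r10, h_r11, h_r12, h_r13, h_r14, h_r15, h_rip, h_fl, hμ]
  all_goals first | exact hHas _ _ | exact hCan _ | exact hNF _ hopt1 | exact Or.inl hfam | exact hQ _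

/-- `shr eax, cl` -/
example (h_rax : u.reg .rax = rax) (h_rcx : u.reg .rcx = rcx) (h_rdx : u.reg .rdx = rdx) (h_rbx : u.reg .rbx = rbx) (h_rsp : u.reg .rsp = rsp) (h_rbp : u.reg .rbp = rbp) (h_rsi : u.reg .rsi = rsi) (h_rdi : u.reg .rdi = rdi) (h_r8 : u.reg .r8 = r8) (h_r9 : u.reg .r9 = r9) (h_r10 : u.reg .r10 = r10) (h_r11 : u.reg .r11 = r11) (h_r12 : u.reg .r12 = r12) (h_r13 : u.reg .r13 = r13) (h_r14 : u.reg .r14 = r14) (h_r15 : u.reg .r15 = r15) (h_rip : u.rip = 0x100000) (h_fl : u.flags = fl) (hμ : μ.vendor = .intel)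
    (hHas : ∀ a n, L.Has a n) (hCan : ∀ a : Word, a < 0x40000000)
    (hNF : ∀ {α : Type} (x : Option α), x ≠ none) (hfam : μ.cfg.field Feature.familyId = 6) (hQ : ∀ v, Q v) :
    InsnGoal L μ u Q (insn% [0xd3, 0xe8]) := by
  u_insn [h_rax, h_rcx, h_rdx, h_rbx, h_rsp, h_rbp, h_rsi, h_rdi, h_r8, h_r9, h_r10, h_r11, h_r12, h_r13, h_r14, h_r15, h_rip, h_fl, hμ]
  all_goals first | exact hHas _ _ | exact hCan _ | exact hNF _ hopt1 | exact Or.inl hfam | exact hQ _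

/-- `sar eax, 0x2` -/
example (h_rax : u.reg .rax = rax) (h_rcx : u.reg .rcx = rcx) (h_rdx : u.reg .rdx = rdx) (h_rbx : u.reg .rbx = rbx) (h_rsp : u.reg .rsp = rsp) (h_rbp : u.reg .rbp = rbp) (h_rsi : u.reg .rsi = rsi) (h_rdi : u.reg .rdi = rdi) (h_r8 : u.reg .r8 = r8) (h_r9 : u.reg .r9 = r9) (h_r10 : u.reg .r10 = r10) (h_r11 : u.reg .r11 = r11) (h_r12 : u.reg .r12 = r12) (h_r13 : u.reg .r13 = r13) (h_r14 : u.reg .r14 = r14) (h_r15 : u.reg .r15 = r15) (h_rip : u.rip = 0x100000) (h_fl : u.flags = fl) (hμ : μ.vendor = .intel)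
    (hHas : ∀ a n, L.Has a n) (hCan : ∀ a : Word, a < 0x40000000)
    (hNF : ∀ {α : Type} (x : Option α), x ≠ none) (hfam : μ.cfg.field Feature.familyId = 6) (hQ : ∀ v, Q v) :
    InsnGoal L μ u Q (insn% [0xc1, 0xf8, 0x02]) := by
  u_insn [h_rax, h_rcx, h_rdx, h_rbx, h_rsp, h_rbp, h_rsi, h_rdi, h_r8, h_r9, h_r10, h_r11, h_r12, h_r13, h_r14, h_r15, h_rip, h_fl, hμ]
  all_goals first | exact hHas _ _ | exact hCan _ | exact hNF _ hopt1 | exact Or.inl hfam | exact hQ _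

/-- `sar ebx, 1` -/
example (h_rax : u.reg .rax = rax) (h_rcx : u.reg .rcx = rcx) (h_rdx : u.reg .rdx = rdx) (h_rbx : u.reg .rbx = rbx) (h_rsp : u.reg .rsp = rsp) (h_rbp : u.reg .rbp = rbp) (h_rsi : u.reg .rsi = rsi) (h_rdi : u.reg .rdi = rdi) (h_r8 : u.reg .r8 = r8) (h_r9 : u.reg .r9 = r9) (h_r10 : u.reg .r10 = r10) (h_r11 : u.reg .r11 = r11) (h_r12 : u.reg .r12 = r12) (h_r13 : u.reg .r13 = r13) (h_r14 : u.reg .r14 = r14) (h_r15 : u.reg .r15 = r15) (h_rip : u.rip = 0x100000) (h_fl : u.flags = fl) (hμ : μ.vendor = .intel)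
    (hHas : ∀ a n, L.Has a n) (hCan : ∀ a : Word, a < 0x40000000)
    (hNF : ∀ {α : Type} (x : Option α), x ≠ none) (hfam : μ.cfg.field Feature.familyId = 6) (hQ : ∀ v, Q v) :
    InsnGoal L μ u Q (insn% [0xd1, 0xfb]) := by
  u_insn [h_rax, h_rcx, h_rdx, h_rbx, h_rsp, h_rbp, h_rsi, h_rdi, h_r8, h_r9, h_r10, h_r11, h_r12, h_r13, h_r14, h_r15, h_rip, h_fl, hμ]
  all_goals first | exact hHas _ _ | exact hCan _ | exact hNF _ hopt1 | exact Or.inl hfam | exact hQ _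

/-- `sar eax, cl` -/
example (h_rax : u.reg .rax = rax) (h_rcx : u.reg .rcx = rcx) (h_rdx : u.reg .rdx = rdx) (h_rbx : u.reg .rbx = rbx) (h_rsp : u.reg .rsp = rsp) (h_rbp : u.reg .rbp = rbp) (h_rsi : u.reg .rsi = rsi) (h_rdi : u.reg .rdi = rdi) (h_r8 : u.reg .r8 = r8) (h_r9 : u.reg .r9 = r9) (h_r10 : u.reg .r10 = r10) (h_r11 : u.reg .r11 = r11) (h_r12 : u.reg .r12 = r12) (h_r13 : u.reg .r13 = r13) (h_r14 : u.reg .r14 = r14) (h_r15 : u.reg .r15 = r15) (h_rip : u.rip = 0x100000) (h_fl : u.flags = fl) (hμ : μ.vendor = .intel)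
    (hHas : ∀ a n, L.Has a n) (hCan : ∀ a : Word, a < 0x40000000)
    (hNF : ∀ {α : Type} (x : Option α), x ≠ none) (hfam : μ.cfg.field Feature.familyId = 6) (hQ : ∀ v, Q v) :
    InsnGoal L μ u Q (insn% [0xd3, 0xf8]) := by
  u_insn [h_rax, h_rcx, h_rdx, h_rbx, h_rsp, h_rbp, h_rsi, h_rdi, h_r8, h_r9, h_r10, h_r11, h_r12, h_r13, h_r14, h_r15, h_rip, h_fl, hμ]
  all_goals first | exact hHas _ _ | exact hCan _ | exact hNF _ hopt1 | exact Or.inl hfam | exact hQ _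

/-- `rol eax, 0x10` -/
example (h_rax : u.reg .rax = rax) (h_rcx : u.reg .rcx = rcx) (h_rdx : u.reg .rdx = rdx) (h_rbx : u.reg .rbx = rbx) (h_rsp : u.reg .rsp = rsp) (h_rbp : u.reg .rbp = rbp) (h_rsi : u.reg .rsi = rsi) (h_rdi : u.reg .rdi = rdi) (h_r8 : u.reg .r8 = r8) (h_r9 : u.reg .r9 = r9) (h_r10 : u.reg .r10 = r10) (h_r11 : u.reg .r11 = r11) (h_r12 : u.reg .r12 = r12) (h_r13 : u.reg .r13 = r13) (h_r14 : u.reg .r14 = r14) (h_r15 : u.reg .r15 = r15) (h_rip : u.rip = 0x100000) (h_fl : u.flags = fl) (hμ : μ.vendor = .intel)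
    (hHas : ∀ a n, L.Has a n) (hCan : ∀ a : Word, a < 0x40000000)
    (hNF : ∀ {α : Type} (x : Option α), x ≠ none) (hfam : μ.cfg.field Feature.familyId = 6) (hQ : ∀ v, Q v) :
    InsnGoal L μ u Q (insn% [0xc1, 0xc0, 0x10]) := by
  u_insn [h_rax, h_rcx, h_rdx, h_rbx, h_rsp, h_rbp, h_rsi, h_rdi, h_r8, h_r9, h_r10, h_r11, h_r12, h_r13, h_r14, h_r15, h_rip, h_fl, hμ]
  all_goals first | exact hHas _ _ | exact hCan _ | exact hNF _ hopt1 | exact Or.inl hfam | exact hQ _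

/-- `cdqe` -/
example (h_rax : u.reg .rax = rax) (h_rcx : u.reg .rcx = rcx) (h_rdx : u.reg .rdx = rdx) (h_rbx : u.reg .rbx = rbx) (h_rsp : u.reg .rsp = rsp) (h_rbp : u.reg .rbp = rbp) (h_rsi : u.reg .rsi = rsi) (h_rdi : u.reg .rdi = rdi) (h_r8 : u.reg .r8 = r8) (h_r9 : u.reg .r9 = r9) (h_r10 : u.reg .r10 = r10) (h_r11 : u.reg .r11 = r11) (h_r12 : u.reg .r12 = r12) (h_r13 : u.reg .r13 = r13) (h_r14 : u.reg .r14 = r14) (h_r15 : u.reg .r15 = r15) (h_rip : u.rip = 0x100000) (h_fl : u.flags = fl) (hμ : μ.vendor = .intel)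
    (hHas : ∀ a n, L.Has a n) (hCan : ∀ a : Word, a < 0x40000000)
    (hNF : ∀ {α : Type} (x : Option α), x ≠ none) (hfam : μ.cfg.field Feature.familyId = 6) (hQ : ∀ v, Q v) :
    InsnGoal L μ u Q (insn% [0x48, 0x98]) := by
  u_insn [h_rax, h_rcx, h_rdx, h_rbx, h_rsp, h_rbp, h_rsi, h_rdi, h_r8, h_r9, h_r10, h_r11, h_r12, h_r13, h_r14, h_r15, h_rip, h_fl, hμ]
  all_goals first | exact hHas _ _ | exact hCan _ | exact hNF _ hopt1 | exact Or.inl hfam | exact hQ _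

/-- `cdq` -/
example (h_rax : u.reg .rax = rax) (h_rcx : u.reg .rcx = rcx) (h_rdx : u.reg .rdx = rdx) (h_rbx : u.reg .rbx = rbx) (h_rsp : u.reg .rsp = rsp) (h_rbp : u.reg .rbp = rbp) (h_rsi : u.reg .rsi = rsi) (h_rdi : u.reg .rdi = rdi) (h_r8 : u.reg .r8 = r8) (h_r9 : u.reg .r9 = r9) (h_r10 : u.reg .r10 = r10) (h_r11 : u.reg .r11 = r11) (h_r12 : u.reg .r12 = r12) (h_r13 : u.reg .r13 = r13) (h_r14 : u.reg .r14 = r14) (h_r15 : u.reg .r15 = r15) (h_rip : u.rip = 0x100000) (h_fl : u.flags = fl) (hμ : μ.vendor = .intel)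
    (hHas : ∀ a n, L.Has a n) (hCan : ∀ a : Word, a < 0x40000000)
    (hNF : ∀ {α : Type} (x : Option α), x ≠ none) (hfam : μ.cfg.field Feature.familyId = 6) (hQ : ∀ v, Q v) :
    InsnGoal L μ u Q (insn% [0x99]) := by
  u_insn [h_rax, h_rcx, h_rdx, h_rbx, h_rsp, h_rbp, h_rsi, h_rdi, h_r8, h_r9, h_r10, h_r11, h_r12, h_r13, h_r14, h_r15, h_rip, h_fl, hμ]
  all_goals first | exact hHas _ _ | exact hCan _ | exact hNF _ hopt1 | exact Or.inl hfam | exact hQ _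

/-- `cqo` -/
example (h_rax : u.reg .rax = rax) (h_rcx : u.reg .rcx = rcx) (h_rdx : u.reg .rdx = rdx) (h_rbx : u.reg .rbx = rbx) (h_rsp : u.reg .rsp = rsp) (h_rbp : u.reg .rbp = rbp) (h_rsi : u.reg .rsi = rsi) (h_rdi : u.reg .rdi = rdi) (h_r8 : u.reg .r8 = r8) (h_r9 : u.reg .r9 = r9) (h_r10 : u.reg .r10 = r10) (h_r11 : u.reg .r11 = r11) (h_r12 : u.reg .r12 = r12) (h_r13 : u.reg .r13 = r13) (h_r14 : u.reg .r14 = r14) (h_r15 : u.reg .r15 = r15) (h_rip : u.rip = 0x100000) (h_fl : u.flags = fl) (hμ : μ.vendor = .intel)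
    (hHas : ∀ a n, L.Has a n) (hCan : ∀ a : Word, a < 0x40000000)
    (hNF : ∀ {α : Type} (x : Option α), x ≠ none) (hfam : μ.cfg.field Feature.familyId = 6) (hQ : ∀ v, Q v) :
    InsnGoal L μ u Q (insn% [0x48, 0x99]) := by
  u_insn [h_rax, h_rcx, h_rdx, h_rbx, h_rsp, h_rbp, h_rsi, h_rdi, h_r8, h_r9, h_r10, h_r11, h_r12, h_r13, h_r14, h_r15, h_rip, h_fl, hμ]
  all_goals first | exact hHas _ _ | exact hCan _ | exact hNF _ hopt1 | exact Or.inl hfam | exact hQ _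

/-- `cwde` -/
example (h_rax : u.reg .rax = rax) (h_rcx : u.reg .rcx = rcx) (h_rdx : u.reg .rdx = rdx) (h_rbx : u.reg .rbx = rbx) (h_rsp : u.reg .rsp = rsp) (h_rbp : u.reg .rbp = rbp) (h_rsi : u.reg .rsi = rsi) (h_rdi : u.reg .rdi = rdi) (h_r8 : u.reg .r8 = r8) (h_r9 : u.reg .r9 = r9) (h_r10 : u.reg .r10 = r10) (h_r11 : u.reg .r11 = r11) (h_r12 : u.reg .r12 = r12) (h_r13 : u.reg .r13 = r13) (h_r14 : u.reg .r14 = r14) (h_r15 : u.reg .r15 = r15) (h_rip : u.rip = 0x100000) (h_fl : u.flags = fl) (hμ : μ.vendor = .intel)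
    (hHas : ∀ a n, L.Has a n) (hCan : ∀ a : Word, a < 0x40000000)
    (hNF : ∀ {α : Type} (x : Option α), x ≠ none) (hfam : μ.cfg.field Feature.familyId = 6) (hQ : ∀ v, Q v) :
    InsnGoal L μ u Q (insn% [0x98]) := by
  u_insn [h_rax, h_rcx, h_rdx, h_rbx, h_rsp, h_rbp, h_rsi, h_rdi, h_r8, h_r9, h_r10, h_r11, h_r12, h_r13, h_r14, h_r15, h_rip, h_fl, hμ]
  all_goals first | exact hHas _ _ | exact hCan _ | exact hNF _ hopt1 | exact Or.inl hfam | exact hQ _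

/-- `div ebx` -/
example (h_rax : u.reg .rax = rax) (h_rcx : u.reg .rcx = rcx) (h_rdx : u.reg .rdx = rdx) (h_rbx : u.reg .rbx = rbx) (h_rsp : u.reg .rsp = rsp) (h_rbp : u.reg .rbp = rbp) (h_rsi : u.reg .rsi = rsi) (h_rdi : u.reg .rdi = rdi) (h_r8 : u.reg .r8 = r8) (h_r9 : u.reg .r9 = r9) (h_r10 : u.reg .r10 = r10) (h_r11 : u.reg .r11 = r11) (h_r12 : u.reg .r12 = r12) (h_r13 : u.reg .r13 = r13) (h_r14 : u.reg .r14 = r14) (h_r15 : u.reg .r15 = r15) (h_rip : u.rip = 0x100000) (h_fl : u.flags = fl) (hμ : μ.vendor = .intel)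
    (hHas : ∀ a n, L.Has a n) (hCan : ∀ a : Word, a < 0x40000000)
    (hNF : ∀ {α : Type} (x : Option α), x ≠ none) (hfam : μ.cfg.field Feature.familyId = 6) (hQ : ∀ v, Q v) :
    InsnGoal L μ u Q (insn% [0xf7, 0xf3]) := by
  u_insn [h_rax, h_rcx, h_rdx, h_rbx, h_rsp, h_rbp, h_rsi, h_rdi, h_r8, h_r9, h_r10, h_r11, h_r12, h_r13, h_r14, h_r15, h_rip, h_fl, hμ]
  all_goals first | exact hHas _ _ | exact hCan _ | exact hNF _ hopt1 | exact Or.inl hfam | exact hQ _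

/-- `div dword ptr [rbx+0x8]` -/
example (h_rax : u.reg .rax = rax) (h_rcx : u.reg .rcx = rcx) (h_rdx : u.reg .rdx = rdx) (h_rbx : u.reg .rbx = rbx) (h_rsp : u.reg .rsp = rsp) (h_rbp : u.reg .rbp = rbp) (h_rsi : u.reg .rsi = rsi) (h_rdi : u.reg .rdi = rdi) (h_r8 : u.reg .r8 = r8) (h_r9 : u.reg .r9 = r9) (h_r10 : u.reg .r10 = r10) (h_r11 : u.reg .r11 = r11) (h_r12 : u.reg .r12 = r12) (h_r13 : u.reg .r13 = r13) (h_r14 : u.reg .r14 = r14) (h_r15 : u.reg .r15 = r15) (h_rip : u.rip = 0x100000) (h_fl : u.flags = fl) (hμ : μ.vendor = .intel)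
    (hHas : ∀ a n, L.Has a n) (hCan : ∀ a : Word, a < 0x40000000)
    (hNF : ∀ {α : Type} (x : Option α), x ≠ none) (hfam : μ.cfg.field Feature.familyId = 6) (hQ : ∀ v, Q v) :
    InsnGoal L μ u Q (insn% [0xf7, 0x73, 0x08]) := by
  u_insn [h_rax, h_rcx, h_rdx, h_rbx, h_rsp, h_rbp, h_rsi, h_rdi, h_r8, h_r9, h_r10, h_r11, h_r12, h_r13, h_r14, h_r15, h_rip, h_fl, hμ]
  all_goals first | exact hHas _ _ | exact hCan _ | exact hNF _ hopt1 | exact Or.inl hfam | exact hQ _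

/-- `idiv ecx` -/
example (h_rax : u.reg .rax = rax) (h_rcx : u.reg .rcx = rcx) (h_rdx : u.reg .rdx = rdx) (h_rbx : u.reg .rbx = rbx) (h_rsp : u.reg .rsp = rsp) (h_rbp : u.reg .rbp = rbp) (h_rsi : u.reg .rsi = rsi) (h_rdi : u.reg .rdi = rdi) (h_r8 : u.reg .r8 = r8) (h_r9 : u.reg .r9 = r9) (h_r10 : u.reg .r10 = r10) (h_r11 : u.reg .r11 = r11) (h_r12 : u.reg .r12 = r12) (h_r13 : u.reg .r13 = r13) (h_r14 : u.reg .r14 = r14) (h_r15 : u.reg .r15 = r15) (h_rip : u.rip = 0x100000) (h_fl : u.flags = fl) (hμ : μ.vendor = .intel)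
    (hHas : ∀ a n, L.Has a n) (hCan : ∀ a : Word, a < 0x40000000)
    (hNF : ∀ {α : Type} (x : Option α), x ≠ none) (hfam : μ.cfg.field Feature.familyId = 6) (hQ : ∀ v, Q v) :
    InsnGoal L μ u Q (insn% [0xf7, 0xf9]) := by
  u_insn [h_rax, h_rcx, h_rdx, h_rbx, h_rsp, h_rbp, h_rsi, h_rdi, h_r8, h_r9, h_r10, h_r11, h_r12, h_r13, h_r14, h_r15, h_rip, h_fl, hμ]
  all_goals first | exact hHas _ _ | exact hCan _ | exact hNF _ hopt1 | exact Or.inl hfam | exact hQ _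

/-- `idiv dword ptr [rbp-0x94]` -/
example (h_rax : u.reg .rax = rax) (h_rcx : u.reg .rcx = rcx) (h_rdx : u.reg .rdx = rdx) (h_rbx : u.reg .rbx = rbx) (h_rsp : u.reg .rsp = rsp) (h_rbp : u.reg .rbp = rbp) (h_rsi : u.reg .rsi = rsi) (h_rdi : u.reg .rdi = rdi) (h_r8 : u.reg .r8 = r8) (h_r9 : u.reg .r9 = r9) (h_r10 : u.reg .r10 = r10) (h_r11 : u.reg .r11 = r11) (h_r12 : u.reg .r12 = r12) (h_r13 : u.reg .r13 = r13) (h_r14 : u.reg .r14 = r14) (h_r15 : u.reg .r15 = r15) (h_rip : u.rip = 0x100000) (h_fl : u.flags = fl) (hμ : μ.vendor = .intel)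
    (hHas : ∀ a n, L.Has a n) (hCan : ∀ a : Word, a < 0x40000000)
    (hNF : ∀ {α : Type} (x : Option α), x ≠ none) (hfam : μ.cfg.field Feature.familyId = 6) (hQ : ∀ v, Q v) :
    InsnGoal L μ u Q (insn% [0xf7, 0xbd, 0x6c, 0xff, 0xff, 0xff]) := by
  u_insn [h_rax, h_rcx, h_rdx, h_rbx, h_rsp, h_rbp, h_rsi, h_rdi, h_r8, h_r9, h_r10, h_r11, h_r12, h_r13, h_r14, h_r15, h_rip, h_fl, hμ]
  all_goals first | exact hHas _ _ | exact hCan _ | exact hNF _ hopt1 | exact Or.inl hfam | exact hQ _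

/-- `idiv rcx` -/
example (h_rax : u.reg .rax = rax) (h_rcx : u.reg .rcx = rcx) (h_rdx : u.reg .rdx = rdx) (h_rbx : u.reg .rbx = rbx) (h_rsp : u.reg .rsp = rsp) (h_rbp : u.reg .rbp = rbp) (h_rsi : u.reg .rsi = rsi) (h_rdi : u.reg .rdi = rdi) (h_r8 : u.reg .r8 = r8) (h_r9 : u.reg .r9 = r9) (h_r10 : u.reg .r10 = r10) (h_r11 : u.reg .r11 = r11) (h_r12 : u.reg .r12 = r12) (h_r13 : u.reg .r13 = r13) (h_r14 : u.reg .r14 = r14) (h_r15 : u.reg .r15 = r15) (h_rip : u.rip = 0x100000) (h_fl : u.flags = fl) (hμ : μ.vendor = .intel)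
    (hHas : ∀ a n, L.Has a n) (hCan : ∀ a : Word, a < 0x40000000)
    (hNF : ∀ {α : Type} (x : Option α), x ≠ none) (hfam : μ.cfg.field Feature.familyId = 6) (hQ : ∀ v, Q v) :
    InsnGoal L μ u Q (insn% [0x48, 0xf7, 0xf9]) := by
  u_insn [h_rax, h_rcx, h_rdx, h_rbx, h_rsp, h_rbp, h_rsi, h_rdi, h_r8, h_r9, h_r10, h_r11, h_r12, h_r13, h_r14, h_r15, h_rip, h_fl, hμ]
  all_goals first | exact hHas _ _ | exact hCan _ | exact hNF _ hopt1 | exact Or.inl hfam | exact hQ _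

/-- `setl al` -/
example (h_rax : u.reg .rax = rax) (h_rcx : u.reg .rcx = rcx) (h_rdx : u.reg .rdx = rdx) (h_rbx : u.reg .rbx = rbx) (h_rsp : u.reg .rsp = rsp) (h_rbp : u.reg .rbp = rbp) (h_rsi : u.reg .rsi = rsi) (h_rdi : u.reg .rdi = rdi) (h_r8 : u.reg .r8 = r8) (h_r9 : u.reg .r9 = r9) (h_r10 : u.reg .r10 = r10) (h_r11 : u.reg .r11 = r11) (h_r12 : u.reg .r12 = r12) (h_r13 : u.reg .r13 = r13) (h_r14 : u.reg .r14 = r14) (h_r15 : u.reg .r15 = r15) (h_rip : u.rip = 0x100000) (h_fl : u.flags = fl) (hμ : μ.vendor = .intel)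
    (hHas : ∀ a n, L.Has a n) (hCan : ∀ a : Word, a < 0x40000000)
    (hNF : ∀ {α : Type} (x : Option α), x ≠ none) (hfam : μ.cfg.field Feature.familyId = 6) (hQ : ∀ v, Q v) :
    InsnGoal L μ u Q (insn% [0x0f, 0x9c, 0xc0]) := by
  u_insn [h_rax, h_rcx, h_rdx, h_rbx, h_rsp, h_rbp, h_rsi, h_rdi, h_r8, h_r9, h_r10, h_r11, h_r12, h_r13, h_r14, h_r15, h_rip, h_fl, hμ]
  all_goals first | exact hHas _ _ | exact hCan _ | exact hNF _ hopt1 | exact Or.inl hfam | exact hQ _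

/-- `sete al` -/
example (h_rax : u.reg .rax = rax) (h_rcx : u.reg .rcx = rcx) (h_rdx : u.reg .rdx = rdx) (h_rbx : u.reg .rbx = rbx) (h_rsp : u.reg .rsp = rsp) (h_rbp : u.reg .rbp = rbp) (h_rsi : u.reg .rsi = rsi) (h_rdi : u.reg .rdi = rdi) (h_r8 : u.reg .r8 = r8) (h_r9 : u.reg .r9 = r9) (h_r10 : u.reg .r10 = r10) (h_r11 : u.reg .r11 = r11) (h_r12 : u.reg .r12 = r12) (h_r13 : u.reg .r13 = r13) (h_r14 : u.reg .r14 = r14) (h_r15 : u.reg .r15 = r15) (h_rip : u.rip = 0x100000) (h_fl : u.flags = fl) (hμ : μ.vendor = .intel)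
    (hHas : ∀ a n, L.Has a n) (hCan : ∀ a : Word, a < 0x40000000)
    (hNF : ∀ {α : Type} (x : Option α), x ≠ none) (hfam : μ.cfg.field Feature.familyId = 6) (hQ : ∀ v, Q v) :
    InsnGoal L μ u Q (insn% [0x0f, 0x94, 0xc0]) := by
  u_insn [h_rax, h_rcx, h_rdx, h_rbx, h_rsp, h_rbp, h_rsi, h_rdi, h_r8, h_r9, h_r10, h_r11, h_r12, h_r13, h_r14, h_r15, h_rip, h_fl, hμ]
  all_goals first | exact hHas _ _ | exact hCan _ | exact hNF _ hopt1 | exact Or.inl hfam | exact hQ _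

/-- `setb dl` -/
example (h_rax : u.reg .rax = rax) (h_rcx : u.reg .rcx = rcx) (h_rdx : u.reg .rdx = rdx) (h_rbx : u.reg .rbx = rbx) (h_rsp : u.reg .rsp = rsp) (h_rbp : u.reg .rbp = rbp) (h_rsi : u.reg .rsi = rsi) (h_rdi : u.reg .rdi = rdi) (h_r8 : u.reg .r8 = r8) (h_r9 : u.reg .r9 = r9) (h_r10 : u.reg .r10 = r10) (h_r11 : u.reg .r11 = r11) (h_r12 : u.reg .r12 = r12) (h_r13 : u.reg .r13 = r13) (h_r14 : u.reg .r14 = r14) (h_r15 : u.reg .r15 = r15) (h_rip : u.rip = 0x100000) (h_fl : u.flags = fl) (hμ : μ.vendor = .intel)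
    (hHas : ∀ a n, L.Has a n) (hCan : ∀ a : Word, a < 0x40000000)
    (hNF : ∀ {α : Type} (x : Option α), x ≠ none) (hfam : μ.cfg.field Feature.familyId = 6) (hQ : ∀ v, Q v) :
    InsnGoal L μ u Q (insn% [0x0f, 0x92, 0xc2]) := by
  u_insn [h_rax, h_rcx, h_rdx, h_rbx, h_rsp, h_rbp, h_rsi, h_rdi, h_r8, h_r9, h_r10, h_r11, h_r12, h_r13, h_r14, h_r15, h_rip, h_fl, hμ]
  all_goals first | exact hHas _ _ | exact hCan _ | exact hNF _ hopt1 | exact Or.inl hfam | exact hQ _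

/-- `setne byte ptr [rbx]` -/
example (h_rax : u.reg .rax = rax) (h_rcx : u.reg .rcx = rcx) (h_rdx : u.reg .rdx = rdx) (h_rbx : u.reg .rbx = rbx) (h_rsp : u.reg .rsp = rsp) (h_rbp : u.reg .rbp = rbp) (h_rsi : u.reg .rsi = rsi) (h_rdi : u.reg .rdi = rdi) (h_r8 : u.reg .r8 = r8) (h_r9 : u.reg .r9 = r9) (h_r10 : u.reg .r10 = r10) (h_r11 : u.reg .r11 = r11) (h_r12 : u.reg .r12 = r12) (h_r13 : u.reg .r13 = r13) (h_r14 : u.reg .r14 = r14) (h_r15 : u.reg .r15 = r15) (h_rip : u.rip = 0x100000) (h_fl : u.flags = fl) (hμ : μ.vendor = .intel)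
    (hHas : ∀ a n, L.Has a n) (hCan : ∀ a : Word, a < 0x40000000)
    (hNF : ∀ {α : Type} (x : Option α), x ≠ none) (hfam : μ.cfg.field Feature.familyId = 6) (hQ : ∀ v, Q v) :
    InsnGoal L μ u Q (insn% [0x0f, 0x95, 0x03]) := by
  u_insn [h_rax, h_rcx, h_rdx, h_rbx, h_rsp, h_rbp, h_rsi, h_rdi, h_r8, h_r9, h_r10, h_r11, h_r12, h_r13, h_r14, h_r15, h_rip, h_fl, hμ]
  all_goals first | exact hHas _ _ | exact hCan _ | exact hNF _ hopt1 | exact Or.inl hfam | exact hQ _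

/-- `cmovns rax, rcx` -/
example (h_rax : u.reg .rax = rax) (h_rcx : u.reg .rcx = rcx) (h_rdx : u.reg .rdx = rdx) (h_rbx : u.reg .rbx = rbx) (h_rsp : u.reg .rsp = rsp) (h_rbp : u.reg .rbp = rbp) (h_rsi : u.reg .rsi = rsi) (h_rdi : u.reg .rdi = rdi) (h_r8 : u.reg .r8 = r8) (h_r9 : u.reg .r9 = r9) (h_r10 : u.reg .r10 = r10) (h_r11 : u.reg .r11 = r11) (h_r12 : u.reg .r12 = r12) (h_r13 : u.reg .r13 = r13) (h_r14 : u.reg .r14 = r14) (h_r15 : u.reg .r15 = r15) (h_rip : u.rip = 0x100000) (h_fl : u.flags = fl) (hμ : μ.vendor = .intel)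
    (hHas : ∀ a n, L.Has a n) (hCan : ∀ a : Word, a < 0x40000000)
    (hNF : ∀ {α : Type} (x : Option α), x ≠ none) (hfam : μ.cfg.field Feature.familyId = 6) (hQ : ∀ v, Q v) :
    InsnGoal L μ u Q (insn% [0x48, 0x0f, 0x49, 0xc1]) := by
  u_insn [h_rax, h_rcx, h_rdx, h_rbx, h_rsp, h_rbp, h_rsi, h_rdi, h_r8, h_r9, h_r10, h_r11, h_r12, h_r13, h_r14, h_r15, h_rip, h_fl, hμ]
  all_goals first | exact hHas _ _ | exact hCan _ | exact hNF _ hopt1 | exact Or.inl hfam | exact hQ _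

/-- `cmova r12d, r13d` -/
example (h_rax : u.reg .rax = rax) (h_rcx : u.reg .rcx = rcx) (h_rdx : u.reg .rdx = rdx) (h_rbx : u.reg .rbx = rbx) (h_rsp : u.reg .rsp = rsp) (h_rbp : u.reg .rbp = rbp) (h_rsi : u.reg .rsi = rsi) (h_rdi : u.reg .rdi = rdi) (h_r8 : u.reg .r8 = r8) (h_r9 : u.reg .r9 = r9) (h_r10 : u.reg .r10 = r10) (h_r11 : u.reg .r11 = r11) (h_r12 : u.reg .r12 = r12) (h_r13 : u.reg .r13 = r13) (h_r14 : u.reg .r14 = r14) (h_r15 : u.reg .r15 = r15) (h_rip : u.rip = 0x100000) (h_fl : u.flags = fl) (hμ : μ.vendor = .intel)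
    (hHas : ∀ a n, L.Has a n) (hCan : ∀ a : Word, a < 0x40000000)
    (hNF : ∀ {α : Type} (x : Option α), x ≠ none) (hfam : μ.cfg.field Feature.familyId = 6) (hQ : ∀ v, Q v) :
    InsnGoal L μ u Q (insn% [0x45, 0x0f, 0x47, 0xe5]) := by
  u_insn [h_rax, h_rcx, h_rdx, h_rbx, h_rsp, h_rbp, h_rsi, h_rdi, h_r8, h_r9, h_r10, h_r11, h_r12, h_r13, h_r14, h_r15, h_rip, h_fl, hμ]
  all_goals first | exact hHas _ _ | exact hCan _ | exact hNF _ hopt1 | exact Or.inl hfam | exact hQ _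

/-- `cmove eax, dword ptr [rsp+4]` -/
example (h_rax : u.reg .rax = rax) (h_rcx : u.reg .rcx = rcx) (h_rdx : u.reg .rdx = rdx) (h_rbx : u.reg .rbx = rbx) (h_rsp : u.reg .rsp = rsp) (h_rbp : u.reg .rbp = rbp) (h_rsi : u.reg .rsi = rsi) (h_rdi : u.reg .rdi = rdi) (h_r8 : u.reg .r8 = r8) (h_r9 : u.reg .r9 = r9) (h_r10 : u.reg .r10 = r10) (h_r11 : u.reg .r11 = r11) (h_r12 : u.reg .r12 = r12) (h_r13 : u.reg .r13 = r13) (h_r14 : u.reg .r14 = r14) (h_r15 : u.reg .r15 = r15) (h_rip : u.rip = 0x100000) (h_fl : u.flags = fl) (hμ : μ.vendor = .intel)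
    (hHas : ∀ a n, L.Has a n) (hCan : ∀ a : Word, a < 0x40000000)
    (hNF : ∀ {α : Type} (x : Option α), x ≠ none) (hfam : μ.cfg.field Feature.familyId = 6) (hQ : ∀ v, Q v) :
    InsnGoal L μ u Q (insn% [0x0f, 0x44, 0x44, 0x24, 0x04]) := by
  u_insn [h_rax, h_rcx, h_rdx, h_rbx, h_rsp, h_rbp, h_rsi, h_rdi, h_r8, h_r9, h_r10, h_r11, h_r12, h_r13, h_r14, h_r15, h_rip, h_fl, hμ]
  all_goals first | exact hHas _ _ | exact hCan _ | exact hNF _ hopt1 | exact Or.inl hfam | exact hQ _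

/-- `je .+0x12` -/
example (h_rax : u.reg .rax = rax) (h_rcx : u.reg .rcx = rcx) (h_rdx : u.reg .rdx = rdx) (h_rbx : u.reg .rbx = rbx) (h_rsp : u.reg .rsp = rsp) (h_rbp : u.reg .rbp = rbp) (h_rsi : u.reg .rsi = rsi) (h_rdi : u.reg .rdi = rdi) (h_r8 : u.reg .r8 = r8) (h_r9 : u.reg .r9 = r9) (h_r10 : u.reg .r10 = r10) (h_r11 : u.reg .r11 = r11) (h_r12 : u.reg .r12 = r12) (h_r13 : u.reg .r13 = r13) (h_r14 : u.reg .r14 = r14) (h_r15 : u.reg .r15 = r15) (h_rip : u.rip = 0x100000) (h_fl : u.flags = fl) (hμ : μ.vendor = .intel)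
    (hHas : ∀ a n, L.Has a n) (hCan : ∀ a : Word, a < 0x40000000)
    (hNF : ∀ {α : Type} (x : Option α), x ≠ none) (hfam : μ.cfg.field Feature.familyId = 6) (hQ : ∀ v, Q v) :
    InsnGoal L μ u Q (insn% [0x74, 0x10]) := by
  u_insn [h_rax, h_rcx, h_rdx, h_rbx, h_rsp, h_rbp, h_rsi, h_rdi, h_r8, h_r9, h_r10, h_r11, h_r12, h_r13, h_r14, h_r15, h_rip, h_fl, hμ]
  all_goals first | exact hHas _ _ | exact hCan _ | exact hNF _ hopt1 | exact Or.inl hfam | exact hQ _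

/-- `jne .-0x10` -/
example (h_rax : u.reg .rax = rax) (h_rcx : u.reg .rcx = rcx) (h_rdx : u.reg .rdx = rdx) (h_rbx : u.reg .rbx = rbx) (h_rsp : u.reg .rsp = rsp) (h_rbp : u.reg .rbp = rbp) (h_rsi : u.reg .rsi = rsi) (h_rdi : u.reg .rdi = rdi) (h_r8 : u.reg .r8 = r8) (h_r9 : u.reg .r9 = r9) (h_r10 : u.reg .r10 = r10) (h_r11 : u.reg .r11 = r11) (h_r12 : u.reg .r12 = r12) (h_r13 : u.reg .r13 = r13) (h_r14 : u.reg .r14 = r14) (h_r15 : u.reg .r15 = r15) (h_rip : u.rip = 0x100000) (h_fl : u.flags = fl) (hμ : μ.vendor = .intel)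
    (hHas : ∀ a n, L.Has a n) (hCan : ∀ a : Word, a < 0x40000000)
    (hNF : ∀ {α : Type} (x : Option α), x ≠ none) (hfam : μ.cfg.field Feature.familyId = 6) (hQ : ∀ v, Q v) :
    InsnGoal L μ u Q (insn% [0x75, 0xee]) := by
  u_insn [h_rax, h_rcx, h_rdx, h_rbx, h_rsp, h_rbp, h_rsi, h_rdi, h_r8, h_r9, h_r10, h_r11, h_r12, h_r13, h_r14, h_r15, h_rip, h_fl, hμ]
  all_goals first | exact hHas _ _ | exact hCan _ | exact hNF _ hopt1 | exact Or.inl hfam | exact hQ _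

/-- `jle .+0x1234` -/
example (h_rax : u.reg .rax = rax) (h_rcx : u.reg .rcx = rcx) (h_rdx : u.reg .rdx = rdx) (h_rbx : u.reg .rbx = rbx) (h_rsp : u.reg .rsp = rsp) (h_rbp : u.reg .rbp = rbp) (h_rsi : u.reg .rsi = rsi) (h_rdi : u.reg .rdi = rdi) (h_r8 : u.reg .r8 = r8) (h_r9 : u.reg .r9 = r9) (h_r10 : u.reg .r10 = r10) (h_r11 : u.reg .r11 = r11) (h_r12 : u.reg .r12 = r12) (h_r13 : u.reg .r13 = r13) (h_r14 : u.reg .r14 = r14) (h_r15 : u.reg .r15 = r15) (h_rip : u.rip = 0x100000) (h_fl : u.flags = fl) (hμ : μ.vendor = .intel)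
    (hHas : ∀ a n, L.Has a n) (hCan : ∀ a : Word, a < 0x40000000)
    (hNF : ∀ {α : Type} (x : Option α), x ≠ none) (hfam : μ.cfg.field Feature.familyId = 6) (hQ : ∀ v, Q v) :
    InsnGoal L μ u Q (insn% [0x0f, 0x8e, 0x2e, 0x12, 0x00, 0x00]) := by
  u_insn [h_rax, h_rcx, h_rdx, h_rbx, h_rsp, h_rbp, h_rsi, h_rdi, h_r8, h_r9, h_r10, h_r11, h_r12, h_r13, h_r14, h_r15, h_rip, h_fl, hμ]
  all_goals first | exact hHas _ _ | exact hCan _ | exact hNF _ hopt1 | exact Or.inl hfam | exact hQ _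

/-- `ja .+0x300` -/
example (h_rax : u.reg .rax = rax) (h_rcx : u.reg .rcx = rcx) (h_rdx : u.reg .rdx = rdx) (h_rbx : u.reg .rbx = rbx) (h_rsp : u.reg .rsp = rsp) (h_rbp : u.reg .rbp = rbp) (h_rsi : u.reg .rsi = rsi) (h_rdi : u.reg .rdi = rdi) (h_r8 : u.reg .r8 = r8) (h_r9 : u.reg .r9 = r9) (h_r10 : u.reg .r10 = r10) (h_r11 : u.reg .r11 = r11) (h_r12 : u.reg .r12 = r12) (h_r13 : u.reg .r13 = r13) (h_r14 : u.reg .r14 = r14) (h_r15 : u.reg .r15 = r15) (h_rip : u.rip = 0x100000) (h_fl : u.flags = fl) (hμ : μ.vendor = .intel)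
    (hHas : ∀ a n, L.Has a n) (hCan : ∀ a : Word, a < 0x40000000)
    (hNF : ∀ {α : Type} (x : Option α), x ≠ none) (hfam : μ.cfg.field Feature.familyId = 6) (hQ : ∀ v, Q v) :
    InsnGoal L μ u Q (insn% [0x0f, 0x87, 0xfa, 0x02, 0x00, 0x00]) := by
  u_insn [h_rax, h_rcx, h_rdx, h_rbx, h_rsp, h_rbp, h_rsi, h_rdi, h_r8, h_r9, h_r10, h_r11, h_r12, h_r13, h_r14, h_r15, h_rip, h_fl, hμ]
  all_goals first | exact hHas _ _ | exact hCan _ | exact hNF _ hopt1 | exact Or.inl hfam | exact hQ _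

/-- `js .+0x8` -/
example (h_rax : u.reg .rax = rax) (h_rcx : u.reg .rcx = rcx) (h_rdx : u.reg .rdx = rdx) (h_rbx : u.reg .rbx = rbx) (h_rsp : u.reg .rsp = rsp) (h_rbp : u.reg .rbp = rbp) (h_rsi : u.reg .rsi = rsi) (h_rdi : u.reg .rdi = rdi) (h_r8 : u.reg .r8 = r8) (h_r9 : u.reg .r9 = r9) (h_r10 : u.reg .r10 = r10) (h_r11 : u.reg .r11 = r11) (h_r12 : u.reg .r12 = r12) (h_r13 : u.reg .r13 = r13) (h_r14 : u.reg .r14 = r14) (h_r15 : u.reg .r15 = r15) (h_rip : u.rip = 0x100000) (h_fl : u.flags = fl) (hμ : μ.vendor = .intel)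
    (hHas : ∀ a n, L.Has a n) (hCan : ∀ a : Word, a < 0x40000000)
    (hNF : ∀ {α : Type} (x : Option α), x ≠ none) (hfam : μ.cfg.field Feature.familyId = 6) (hQ : ∀ v, Q v) :
    InsnGoal L μ u Q (insn% [0x78, 0x06]) := by
  u_insn [h_rax, h_rcx, h_rdx, h_rbx, h_rsp, h_rbp, h_rsi, h_rdi, h_r8, h_r9, h_r10, h_r11, h_r12, h_r13, h_r14, h_r15, h_rip, h_fl, hμ]
  all_goals first | exact hHas _ _ | exact hCan _ | exact hNF _ hopt1 | exact Or.inl hfam | exact hQ _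

/-- `jmp .-0x1` -/
example (h_rax : u.reg .rax = rax) (h_rcx : u.reg .rcx = rcx) (h_rdx : u.reg .rdx = rdx) (h_rbx : u.reg .rbx = rbx) (h_rsp : u.reg .rsp = rsp) (h_rbp : u.reg .rbp = rbp) (h_rsi : u.reg .rsi = rsi) (h_rdi : u.reg .rdi = rdi) (h_r8 : u.reg .r8 = r8) (h_r9 : u.reg .r9 = r9) (h_r10 : u.reg .r10 = r10) (h_r11 : u.reg .r11 = r11) (h_r12 : u.reg .r12 = r12) (h_r13 : u.reg .r13 = r13) (h_r14 : u.reg .r14 = r14) (h_r15 : u.reg .r15 = r15) (h_rip : u.rip = 0x100000) (h_fl : u.flags = fl) (hμ : μ.vendor = .intel)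
    (hHas : ∀ a n, L.Has a n) (hCan : ∀ a : Word, a < 0x40000000)
    (hNF : ∀ {α : Type} (x : Option α), x ≠ none) (hfam : μ.cfg.field Feature.familyId = 6) (hQ : ∀ v, Q v) :
    InsnGoal L μ u Q (insn% [0xeb, 0xfd]) := by
  u_insn [h_rax, h_rcx, h_rdx, h_rbx, h_rsp, h_rbp, h_rsi, h_rdi, h_r8, h_r9, h_r10, h_r11, h_r12, h_r13, h_r14, h_r15, h_rip, h_fl, hμ]
  all_goals first | exact hHas _ _ | exact hCan _ | exact hNF _ hopt1 | exact Or.inl hfam | exact hQ _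

/-- `jmp .+0x1000` -/
example (h_rax : u.reg .rax = rax) (h_rcx : u.reg .rcx = rcx) (h_rdx : u.reg .rdx = rdx) (h_rbx : u.reg .rbx = rbx) (h_rsp : u.reg .rsp = rsp) (h_rbp : u.reg .rbp = rbp) (h_rsi : u.reg .rsi = rsi) (h_rdi : u.reg .rdi = rdi) (h_r8 : u.reg .r8 = r8) (h_r9 : u.reg .r9 = r9) (h_r10 : u.reg .r10 = r10) (h_r11 : u.reg .r11 = r11) (h_r12 : u.reg .r12 = r12) (h_r13 : u.reg .r13 = r13) (h_r14 : u.reg .r14 = r14) (h_r15 : u.reg .r15 = r15) (h_rip : u.rip = 0x100000) (h_fl : u.flags = fl) (hμ : μ.vendor = .intel)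
    (hHas : ∀ a n, L.Has a n) (hCan : ∀ a : Word, a < 0x40000000)
    (hNF : ∀ {α : Type} (x : Option α), x ≠ none) (hfam : μ.cfg.field Feature.familyId = 6) (hQ : ∀ v, Q v) :
    InsnGoal L μ u Q (insn% [0xe9, 0xfb, 0x0f, 0x00, 0x00]) := by
  u_insn [h_rax, h_rcx, h_rdx, h_rbx, h_rsp, h_rbp, h_rsi, h_rdi, h_r8, h_r9, h_r10, h_r11, h_r12, h_r13, h_r14, h_r15, h_rip, h_fl, hμ]
  all_goals first | exact hHas _ _ | exact hCan _ | exact hNF _ hopt1 | exact Or.inl hfam | exact hQ _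

/-- `jmp rax` -/
example (h_rax : u.reg .rax = rax) (h_rcx : u.reg .rcx = rcx) (h_rdx : u.reg .rdx = rdx) (h_rbx : u.reg .rbx = rbx) (h_rsp : u.reg .rsp = rsp) (h_rbp : u.reg .rbp = rbp) (h_rsi : u.reg .rsi = rsi) (h_rdi : u.reg .rdi = rdi) (h_r8 : u.reg .r8 = r8) (h_r9 : u.reg .r9 = r9) (h_r10 : u.reg .r10 = r10) (h_r11 : u.reg .r11 = r11) (h_r12 : u.reg .r12 = r12) (h_r13 : u.reg .r13 = r13) (h_r14 : u.reg .r14 = r14) (h_r15 : u.reg .r15 = r15) (h_rip : u.rip = 0x100000) (h_fl : u.flags = fl) (hμ : μ.vendor = .intel)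
    (hHas : ∀ a n, L.Has a n) (hCan : ∀ a : Word, a < 0x40000000)
    (hNF : ∀ {α : Type} (x : Option α), x ≠ none) (hfam : μ.cfg.field Feature.familyId = 6) (hQ : ∀ v, Q v) :
    InsnGoal L μ u Q (insn% [0xff, 0xe0]) := by
  u_insn [h_rax, h_rcx, h_rdx, h_rbx, h_rsp, h_rbp, h_rsi, h_rdi, h_r8, h_r9, h_r10, h_r11, h_r12, h_r13, h_r14, h_r15, h_rip, h_fl, hμ]
  all_goals first | exact hHas _ _ | exact hCan _ | exact hNF _ hopt1 | exact Or.inl hfam | exact hQ _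

/-- `jmp qword ptr [rax*8+0x120000]` -/
example (h_rax : u.reg .rax = rax) (h_rcx : u.reg .rcx = rcx) (h_rdx : u.reg .rdx = rdx) (h_rbx : u.reg .rbx = rbx) (h_rsp : u.reg .rsp = rsp) (h_rbp : u.reg .rbp = rbp) (h_rsi : u.reg .rsi = rsi) (h_rdi : u.reg .rdi = rdi) (h_r8 : u.reg .r8 = r8) (h_r9 : u.reg .r9 = r9) (h_r10 : u.reg .r10 = r10) (h_r11 : u.reg .r11 = r11) (h_r12 : u.reg .r12 = r12) (h_r13 : u.reg .r13 = r13) (h_r14 : u.reg .r14 = r14) (h_r15 : u.reg .r15 = r15) (h_rip : u.rip = 0x100000) (h_fl : u.flags = fl) (hμ : μ.vendor = .intel)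
    (hHas : ∀ a n, L.Has a n) (hCan : ∀ a : Word, a < 0x40000000)
    (hNF : ∀ {α : Type} (x : Option α), x ≠ none) (hfam : μ.cfg.field Feature.familyId = 6) (hQ : ∀ v, Q v) :
    InsnGoal L μ u Q (insn% [0xff, 0x24, 0xc5, 0x00, 0x00, 0x12, 0x00]) := by
  u_insn [h_rax, h_rcx, h_rdx, h_rbx, h_rsp, h_rbp, h_rsi, h_rdi, h_r8, h_r9, h_r10, h_r11, h_r12, h_r13, h_r14, h_r15, h_rip, h_fl, hμ]
  all_goals first | exact hHas _ _ | exact hCan _ | exact hNF _ hopt1 | exact Or.inl hfam | exact hQ _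

/-- `call .+0xbc78` -/
example (h_rax : u.reg .rax = rax) (h_rcx : u.reg .rcx = rcx) (h_rdx : u.reg .rdx = rdx) (h_rbx : u.reg .rbx = rbx) (h_rsp : u.reg .rsp = rsp) (h_rbp : u.reg .rbp = rbp) (h_rsi : u.reg .rsi = rsi) (h_rdi : u.reg .rdi = rdi) (h_r8 : u.reg .r8 = r8) (h_r9 : u.reg .r9 = r9) (h_r10 : u.reg .r10 = r10) (h_r11 : u.reg .r11 = r11) (h_r12 : u.reg .r12 = r12) (h_r13 : u.reg .r13 = r13) (h_r14 : u.reg .r14 = r14) (h_r15 : u.reg .r15 = r15) (h_rip : u.rip = 0x100000) (h_fl : u.flags = fl) (hμ : μ.vendor = .intel)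
    (hHas : ∀ a n, L.Has a n) (hCan : ∀ a : Word, a < 0x40000000)
    (hNF : ∀ {α : Type} (x : Option α), x ≠ none) (hfam : μ.cfg.field Feature.familyId = 6) (hQ : ∀ v, Q v) :
    InsnGoal L μ u Q (insn% [0xe8, 0x73, 0xbc, 0x00, 0x00]) := by
  u_insn [h_rax, h_rcx, h_rdx, h_rbx, h_rsp, h_rbp, h_rsi, h_rdi, h_r8, h_r9, h_r10, h_r11, h_r12, h_r13, h_r14, h_r15, h_rip, h_fl, hμ]
  all_goals first | exact hHas _ _ | exact hCan _ | exact hNF _ hopt1 | exact Or.inl hfam | exact hQ _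

/-- `call rax` -/
example (h_rax : u.reg .rax = rax) (h_rcx : u.reg .rcx = rcx) (h_rdx : u.reg .rdx = rdx) (h_rbx : u.reg .rbx = rbx) (h_rsp : u.reg .rsp = rsp) (h_rbp : u.reg .rbp = rbp) (h_rsi : u.reg .rsi = rsi) (h_rdi : u.reg .rdi = rdi) (h_r8 : u.reg .r8 = r8) (h_r9 : u.reg .r9 = r9) (h_r10 : u.reg .r10 = r10) (h_r11 : u.reg .r11 = r11) (h_r12 : u.reg .r12 = r12) (h_r13 : u.reg .r13 = r13) (h_r14 : u.reg .r14 = r14) (h_r15 : u.reg .r15 = r15) (h_rip : u.rip = 0x100000) (h_fl : u.flags = fl) (hμ : μ.vendor = .intel)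
    (hHas : ∀ a n, L.Has a n) (hCan : ∀ a : Word, a < 0x40000000)
    (hNF : ∀ {α : Type} (x : Option α), x ≠ none) (hfam : μ.cfg.field Feature.familyId = 6) (hQ : ∀ v, Q v) :
    InsnGoal L μ u Q (insn% [0xff, 0xd0]) := by
  u_insn [h_rax, h_rcx, h_rdx, h_rbx, h_rsp, h_rbp, h_rsi, h_rdi, h_r8, h_r9, h_r10, h_r11, h_r12, h_r13, h_r14, h_r15, h_rip, h_fl, hμ]
  all_goals first | exact hHas _ _ | exact hCan _ | exact hNF _ hopt1 | exact Or.inl hfam | exact hQ _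

/-- `call qword ptr [rbx]` -/
example (h_rax : u.reg .rax = rax) (h_rcx : u.reg .rcx = rcx) (h_rdx : u.reg .rdx = rdx) (h_rbx : u.reg .rbx = rbx) (h_rsp : u.reg .rsp = rsp) (h_rbp : u.reg .rbp = rbp) (h_rsi : u.reg .rsi = rsi) (h_rdi : u.reg .rdi = rdi) (h_r8 : u.reg .r8 = r8) (h_r9 : u.reg .r9 = r9) (h_r10 : u.reg .r10 = r10) (h_r11 : u.reg .r11 = r11) (h_r12 : u.reg .r12 = r12) (h_r13 : u.reg .r13 = r13) (h_r14 : u.reg .r14 = r14) (h_r15 : u.reg .r15 = r15) (h_rip : u.rip = 0x100000) (h_fl : u.flags = fl) (hμ : μ.vendor = .intel)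
    (hHas : ∀ a n, L.Has a n) (hCan : ∀ a : Word, a < 0x40000000)
    (hNF : ∀ {α : Type} (x : Option α), x ≠ none) (hfam : μ.cfg.field Feature.familyId = 6) (hQ : ∀ v, Q v) :
    InsnGoal L μ u Q (insn% [0xff, 0x13]) := by
  u_insn [h_rax, h_rcx, h_rdx, h_rbx, h_rsp, h_rbp, h_rsi, h_rdi, h_r8, h_r9, h_r10, h_r11, h_r12, h_r13, h_r14, h_r15, h_rip, h_fl, hμ]
  all_goals first | exact hHas _ _ | exact hCan _ | exact hNF _ hopt1 | exact Or.inl hfam | exact hQ _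

/-- `ret` -/
example (h_rax : u.reg .rax = rax) (h_rcx : u.reg .rcx = rcx) (h_rdx : u.reg .rdx = rdx) (h_rbx : u.reg .rbx = rbx) (h_rsp : u.reg .rsp = rsp) (h_rbp : u.reg .rbp = rbp) (h_rsi : u.reg .rsi = rsi) (h_rdi : u.reg .rdi = rdi) (h_r8 : u.reg .r8 = r8) (h_r9 : u.reg .r9 = r9) (h_r10 : u.reg .r10 = r10) (h_r11 : u.reg .r11 = r11) (h_r12 : u.reg .r12 = r12) (h_r13 : u.reg .r13 = r13) (h_r14 : u.reg .r14 = r14) (h_r15 : u.reg .r15 = r15) (h_rip : u.rip = 0x100000) (h_fl : u.flags = fl) (hμ : μ.vendor = .intel)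
    (hHas : ∀ a n, L.Has a n) (hCan : ∀ a : Word, a < 0x40000000)
    (hNF : ∀ {α : Type} (x : Option α), x ≠ none) (hfam : μ.cfg.field Feature.familyId = 6) (hQ : ∀ v, Q v) :
    InsnGoal L μ u Q (insn% [0xc3]) := by
  u_insn [h_rax, h_rcx, h_rdx, h_rbx, h_rsp, h_rbp, h_rsi, h_rdi, h_r8, h_r9, h_r10, h_r11, h_r12, h_r13, h_r14, h_r15, h_rip, h_fl, hμ]
  all_goals first | exact hHas _ _ | exact hCan _ | exact hNF _ hopt1 | exact Or.inl hfam | exact hQ _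

/-- `ret 0x10` -/
example (h_rax : u.reg .rax = rax) (h_rcx : u.reg .rcx = rcx) (h_rdx : u.reg .rdx = rdx) (h_rbx : u.reg .rbx = rbx) (h_rsp : u.reg .rsp = rsp) (h_rbp : u.reg .rbp = rbp) (h_rsi : u.reg .rsi = rsi) (h_rdi : u.reg .rdi = rdi) (h_r8 : u.reg .r8 = r8) (h_r9 : u.reg .r9 = r9) (h_r10 : u.reg .r10 = r10) (h_r11 : u.reg .r11 = r11) (h_r12 : u.reg .r12 = r12) (h_r13 : u.reg .r13 = r13) (h_r14 : u.reg .r14 = r14) (h_r15 : u.reg .r15 = r15) (h_rip : u.rip = 0x100000) (h_fl : u.flags = fl) (hμ : μ.vendor = .intel)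
    (hHas : ∀ a n, L.Has a n) (hCan : ∀ a : Word, a < 0x40000000)
    (hNF : ∀ {α : Type} (x : Option α), x ≠ none) (hfam : μ.cfg.field Feature.familyId = 6) (hQ : ∀ v, Q v) :
    InsnGoal L μ u Q (insn% [0xc2, 0x10, 0x00]) := by
  u_insn [h_rax, h_rcx, h_rdx, h_rbx, h_rsp, h_rbp, h_rsi, h_rdi, h_r8, h_r9, h_r10, h_r11, h_r12, h_r13, h_r14, h_r15, h_rip, h_fl, hμ]
  all_goals first | exact hHas _ _ | exact hCan _ | exact hNF _ hopt1 | exact Or.inl hfam | exact hQ _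

/-- `push rbx` -/
example (h_rax : u.reg .rax = rax) (h_rcx : u.reg .rcx = rcx) (h_rdx : u.reg .rdx = rdx) (h_rbx : u.reg .rbx = rbx) (h_rsp : u.reg .rsp = rsp) (h_rbp : u.reg .rbp = rbp) (h_rsi : u.reg .rsi = rsi) (h_rdi : u.reg .rdi = rdi) (h_r8 : u.reg .r8 = r8) (h_r9 : u.reg .r9 = r9) (h_r10 : u.reg .r10 = r10) (h_r11 : u.reg .r11 = r11) (h_r12 : u.reg .r12 = r12) (h_r13 : u.reg .r13 = r13) (h_r14 : u.reg .r14 = r14) (h_r15 : u.reg .r15 = r15) (h_rip : u.rip = 0x100000) (h_fl : u.flags = fl) (hμ : μ.vendor = .intel)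
    (hHas : ∀ a n, L.Has a n) (hCan : ∀ a : Word, a < 0x40000000)
    (hNF : ∀ {α : Type} (x : Option α), x ≠ none) (hfam : μ.cfg.field Feature.familyId = 6) (hQ : ∀ v, Q v) :
    InsnGoal L μ u Q (insn% [0x53]) := by
  u_insn [h_rax, h_rcx, h_rdx, h_rbx, h_rsp, h_rbp, h_rsi, h_rdi, h_r8, h_r9, h_r10, h_r11, h_r12, h_r13, h_r14, h_r15, h_rip, h_fl, hμ]
  all_goals first | exact hHas _ _ | exact hCan _ | exact hNF _ hopt1 | exact Or.inl hfam | exact hQ _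

/-- `push r12` -/
example (h_rax : u.reg .rax = rax) (h_rcx : u.reg .rcx = rcx) (h_rdx : u.reg .rdx = rdx) (h_rbx : u.reg .rbx = rbx) (h_rsp : u.reg .rsp = rsp) (h_rbp : u.reg .rbp = rbp) (h_rsi : u.reg .rsi = rsi) (h_rdi : u.reg .rdi = rdi) (h_r8 : u.reg .r8 = r8) (h_r9 : u.reg .r9 = r9) (h_r10 : u.reg .r10 = r10) (h_r11 : u.reg .r11 = r11) (h_r12 : u.reg .r12 = r12) (h_r13 : u.reg .r13 = r13) (h_r14 : u.reg .r14 = r14) (h_r15 : u.reg .r15 = r15) (h_rip : u.rip = 0x100000) (h_fl : u.flags = fl) (hμ : μ.vendor = .intel)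
    (hHas : ∀ a n, L.Has a n) (hCan : ∀ a : Word, a < 0x40000000)
    (hNF : ∀ {α : Type} (x : Option α), x ≠ none) (hfam : μ.cfg.field Feature.familyId = 6) (hQ : ∀ v, Q v) :
    InsnGoal L μ u Q (insn% [0x41, 0x54]) := by
  u_insn [h_rax, h_rcx, h_rdx, h_rbx, h_rsp, h_rbp, h_rsi, h_rdi, h_r8, h_r9, h_r10, h_r11, h_r12, h_r13, h_r14, h_r15, h_rip, h_fl, hμ]
  all_goals first | exact hHas _ _ | exact hCan _ | exact hNF _ hopt1 | exact Or.inl hfam | exact hQ _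

/-- `push 0x10` -/
example (h_rax : u.reg .rax = rax) (h_rcx : u.reg .rcx = rcx) (h_rdx : u.reg .rdx = rdx) (h_rbx : u.reg .rbx = rbx) (h_rsp : u.reg .rsp = rsp) (h_rbp : u.reg .rbp = rbp) (h_rsi : u.reg .rsi = rsi) (h_rdi : u.reg .rdi = rdi) (h_r8 : u.reg .r8 = r8) (h_r9 : u.reg .r9 = r9) (h_r10 : u.reg .r10 = r10) (h_r11 : u.reg .r11 = r11) (h_r12 : u.reg .r12 = r12) (h_r13 : u.reg .r13 = r13) (h_r14 : u.reg .r14 = r14) (h_r15 : u.reg .r15 = r15) (h_rip : u.rip = 0x100000) (h_fl : u.flags = fl) (hμ : μ.vendor = .intel)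
    (hHas : ∀ a n, L.Has a n) (hCan : ∀ a : Word, a < 0x40000000)
    (hNF : ∀ {α : Type} (x : Option α), x ≠ none) (hfam : μ.cfg.field Feature.familyId = 6) (hQ : ∀ v, Q v) :
    InsnGoal L μ u Q (insn% [0x6a, 0x10]) := by
  u_insn [h_rax, h_rcx, h_rdx, h_rbx, h_rsp, h_rbp, h_rsi, h_rdi, h_r8, h_r9, h_r10, h_r11, h_r12, h_r13, h_r14, h_r15, h_rip, h_fl, hμ]
  all_goals first | exact hHas _ _ | exact hCan _ | exact hNF _ hopt1 | exact Or.inl hfam | exact hQ _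

/-- `push qword ptr [rax]` -/
example (h_rax : u.reg .rax = rax) (h_rcx : u.reg .rcx = rcx) (h_rdx : u.reg .rdx = rdx) (h_rbx : u.reg .rbx = rbx) (h_rsp : u.reg .rsp = rsp) (h_rbp : u.reg .rbp = rbp) (h_rsi : u.reg .rsi = rsi) (h_rdi : u.reg .rdi = rdi) (h_r8 : u.reg .r8 = r8) (h_r9 : u.reg .r9 = r9) (h_r10 : u.reg .r10 = r10) (h_r11 : u.reg .r11 = r11) (h_r12 : u.reg .r12 = r12) (h_r13 : u.reg .r13 = r13) (h_r14 : u.reg .r14 = r14) (h_r15 : u.reg .r15 = r15) (h_rip : u.rip = 0x100000) (h_fl : u.flags = fl) (hμ : μ.vendor = .intel)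
    (hHas : ∀ a n, L.Has a n) (hCan : ∀ a : Word, a < 0x40000000)
    (hNF : ∀ {α : Type} (x : Option α), x ≠ none) (hfam : μ.cfg.field Feature.familyId = 6) (hQ : ∀ v, Q v) :
    InsnGoal L μ u Q (insn% [0xff, 0x30]) := by
  u_insn [h_rax, h_rcx, h_rdx, h_rbx, h_rsp, h_rbp, h_rsi, h_rdi, h_r8, h_r9, h_r10, h_r11, h_r12, h_r13, h_r14, h_r15, h_rip, h_fl, hμ]
  all_goals first | exact hHas _ _ | exact hCan _ | exact hNF _ hopt1 | exact Or.inl hfam | exact hQ _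

/-- `pop rbx` -/
example (h_rax : u.reg .rax = rax) (h_rcx : u.reg .rcx = rcx) (h_rdx : u.reg .rdx = rdx) (h_rbx : u.reg .rbx = rbx) (h_rsp : u.reg .rsp = rsp) (h_rbp : u.reg .rbp = rbp) (h_rsi : u.reg .rsi = rsi) (h_rdi : u.reg .rdi = rdi) (h_r8 : u.reg .r8 = r8) (h_r9 : u.reg .r9 = r9) (h_r10 : u.reg .r10 = r10) (h_r11 : u.reg .r11 = r11) (h_r12 : u.reg .r12 = r12) (h_r13 : u.reg .r13 = r13) (h_r14 : u.reg .r14 = r14) (h_r15 : u.reg .r15 = r15) (h_rip : u.rip = 0x100000) (h_fl : u.flags = fl) (hμ : μ.vendor = .intel)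
    (hHas : ∀ a n, L.Has a n) (hCan : ∀ a : Word, a < 0x40000000)
    (hNF : ∀ {α : Type} (x : Option α), x ≠ none) (hfam : μ.cfg.field Feature.familyId = 6) (hQ : ∀ v, Q v) :
    InsnGoal L μ u Q (insn% [0x5b]) := by
  u_insn [h_rax, h_rcx, h_rdx, h_rbx, h_rsp, h_rbp, h_rsi, h_rdi, h_r8, h_r9, h_r10, h_r11, h_r12, h_r13, h_r14, h_r15, h_rip, h_fl, hμ]
  all_goals first | exact hHas _ _ | exact hCan _ | exact hNF _ hopt1 | exact Or.inl hfam | exact hQ _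

/-- `pop r14` -/
example (h_rax : u.reg .rax = rax) (h_rcx : u.reg .rcx = rcx) (h_rdx : u.reg .rdx = rdx) (h_rbx : u.reg .rbx = rbx) (h_rsp : u.reg .rsp = rsp) (h_rbp : u.reg .rbp = rbp) (h_rsi : u.reg .rsi = rsi) (h_rdi : u.reg .rdi = rdi) (h_r8 : u.reg .r8 = r8) (h_r9 : u.reg .r9 = r9) (h_r10 : u.reg .r10 = r10) (h_r11 : u.reg .r11 = r11) (h_r12 : u.reg .r12 = r12) (h_r13 : u.reg .r13 = r13) (h_r14 : u.reg .r14 = r14) (h_r15 : u.reg .r15 = r15) (h_rip : u.rip = 0x100000) (h_fl : u.flags = fl) (hμ : μ.vendor = .intel)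
    (hHas : ∀ a n, L.Has a n) (hCan : ∀ a : Word, a < 0x40000000)
    (hNF : ∀ {α : Type} (x : Option α), x ≠ none) (hfam : μ.cfg.field Feature.familyId = 6) (hQ : ∀ v, Q v) :
    InsnGoal L μ u Q (insn% [0x41, 0x5e]) := by
  u_insn [h_rax, h_rcx, h_rdx, h_rbx, h_rsp, h_rbp, h_rsi, h_rdi, h_r8, h_r9, h_r10, h_r11, h_r12, h_r13, h_r14, h_r15, h_rip, h_fl, hμ]
  all_goals first | exact hHas _ _ | exact hCan _ | exact hNF _ hopt1 | exact Or.inl hfam | exact hQ _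

/-- `leave` -/
example (h_rax : u.reg .rax = rax) (h_rcx : u.reg .rcx = rcx) (h_rdx : u.reg .rdx = rdx) (h_rbx : u.reg .rbx = rbx) (h_rsp : u.reg .rsp = rsp) (h_rbp : u.reg .rbp = rbp) (h_rsi : u.reg .rsi = rsi) (h_rdi : u.reg .rdi = rdi) (h_r8 : u.reg .r8 = r8) (h_r9 : u.reg .r9 = r9) (h_r10 : u.reg .r10 = r10) (h_r11 : u.reg .r11 = r11) (h_r12 : u.reg .r12 = r12) (h_r13 : u.reg .r13 = r13) (h_r14 : u.reg .r14 = r14) (h_r15 : u.reg .r15 = r15) (h_rip : u.rip = 0x100000) (h_fl : u.flags = fl) (hμ : μ.vendor = .intel)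
    (hHas : ∀ a n, L.Has a n) (hCan : ∀ a : Word, a < 0x40000000)
    (hNF : ∀ {α : Type} (x : Option α), x ≠ none) (hfam : μ.cfg.field Feature.familyId = 6) (hQ : ∀ v, Q v) :
    InsnGoal L μ u Q (insn% [0xc9]) := by
  u_insn [h_rax, h_rcx, h_rdx, h_rbx, h_rsp, h_rbp, h_rsi, h_rdi, h_r8, h_r9, h_r10, h_r11, h_r12, h_r13, h_r14, h_r15, h_rip, h_fl, hμ]
  all_goals first | exact hHas _ _ | exact hCan _ | exact hNF _ hopt1 | exact Or.inl hfam | exact hQ _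

/-- `nop` -/
example (h_rax : u.reg .rax = rax) (h_rcx : u.reg .rcx = rcx) (h_rdx : u.reg .rdx = rdx) (h_rbx : u.reg .rbx = rbx) (h_rsp : u.reg .rsp = rsp) (h_rbp : u.reg .rbp = rbp) (h_rsi : u.reg .rsi = rsi) (h_rdi : u.reg .rdi = rdi) (h_r8 : u.reg .r8 = r8) (h_r9 : u.reg .r9 = r9) (h_r10 : u.reg .r10 = r10) (h_r11 : u.reg .r11 = r11) (h_r12 : u.reg .r12 = r12) (h_r13 : u.reg .r13 = r13) (h_r14 : u.reg .r14 = r14) (h_r15 : u.reg .r15 = r15) (h_rip : u.rip = 0x100000) (h_fl : u.flags = fl) (hμ : μ.vendor = .intel)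
    (hHas : ∀ a n, L.Has a n) (hCan : ∀ a : Word, a < 0x40000000)
    (hNF : ∀ {α : Type} (x : Option α), x ≠ none) (hfam : μ.cfg.field Feature.familyId = 6) (hQ : ∀ v, Q v) :
    InsnGoal L μ u Q (insn% [0x90]) := by
  u_insn [h_rax, h_rcx, h_rdx, h_rbx, h_rsp, h_rbp, h_rsi, h_rdi, h_r8, h_r9, h_r10, h_r11, h_r12, h_r13, h_r14, h_r15, h_rip, h_fl, hμ]
  all_goals first | exact hHas _ _ | exact hCan _ | exact hNF _ hopt1 | exact Or.inl hfam | exact hQ _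

/-- `nop dword ptr [rax+rax*1+0x0]` -/
example (h_rax : u.reg .rax = rax) (h_rcx : u.reg .rcx = rcx) (h_rdx : u.reg .rdx = rdx) (h_rbx : u.reg .rbx = rbx) (h_rsp : u.reg .rsp = rsp) (h_rbp : u.reg .rbp = rbp) (h_rsi : u.reg .rsi = rsi) (h_rdi : u.reg .rdi = rdi) (h_r8 : u.reg .r8 = r8) (h_r9 : u.reg .r9 = r9) (h_r10 : u.reg .r10 = r10) (h_r11 : u.reg .r11 = r11) (h_r12 : u.reg .r12 = r12) (h_r13 : u.reg .r13 = r13) (h_r14 : u.reg .r14 = r14) (h_r15 : u.reg .r15 = r15) (h_rip : u.rip = 0x100000) (h_fl : u.flags = fl) (hμ : μ.vendor = .intel)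
    (hHas : ∀ a n, L.Has a n) (hCan : ∀ a : Word, a < 0x40000000)
    (hNF : ∀ {α : Type} (x : Option α), x ≠ none) (hfam : μ.cfg.field Feature.familyId = 6) (hQ : ∀ v, Q v) :
    InsnGoal L μ u Q (insn% [0x0f, 0x1f, 0x04, 0x00]) := by
  u_insn [h_rax, h_rcx, h_rdx, h_rbx, h_rsp, h_rbp, h_rsi, h_rdi, h_r8, h_r9, h_r10, h_r11, h_r12, h_r13, h_r14, h_r15, h_rip, h_fl, hμ]
  all_goals first | exact hHas _ _ | exact hCan _ | exact hNF _ hopt1 | exact Or.inl hfam | exact hQ _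

/-- `nop word ptr cs:[rax+rax*1+0x0]` -/
example (h_rax : u.reg .rax = rax) (h_rcx : u.reg .rcx = rcx) (h_rdx : u.reg .rdx = rdx) (h_rbx : u.reg .rbx = rbx) (h_rsp : u.reg .rsp = rsp) (h_rbp : u.reg .rbp = rbp) (h_rsi : u.reg .rsi = rsi) (h_rdi : u.reg .rdi = rdi) (h_r8 : u.reg .r8 = r8) (h_r9 : u.reg .r9 = r9) (h_r10 : u.reg .r10 = r10) (h_r11 : u.reg .r11 = r11) (h_r12 : u.reg .r12 = r12) (h_r13 : u.reg .r13 = r13) (h_r14 : u.reg .r14 = r14) (h_r15 : u.reg .r15 = r15) (h_rip : u.rip = 0x100000) (h_fl : u.flags = fl) (hμ : μ.vendor = .intel)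
    (hHas : ∀ a n, L.Has a n) (hCan : ∀ a : Word, a < 0x40000000)
    (hNF : ∀ {α : Type} (x : Option α), x ≠ none) (hfam : μ.cfg.field Feature.familyId = 6) (hQ : ∀ v, Q v) :
    InsnGoal L μ u Q (insn% [0x2e, 0x66, 0x0f, 0x1f, 0x04, 0x00]) := by
  u_insn [h_rax, h_rcx, h_rdx, h_rbx, h_rsp, h_rbp, h_rsi, h_rdi, h_r8, h_r9, h_r10, h_r11, h_r12, h_r13, h_r14, h_r15, h_rip, h_fl, hμ]
  all_goals first | exact hHas _ _ | exact hCan _ | exact hNF _ hopt1 | exact Or.inl hfam | exact hQ _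

/-- `endbr64` -/
example (h_rax : u.reg .rax = rax) (h_rcx : u.reg .rcx = rcx) (h_rdx : u.reg .rdx = rdx) (h_rbx : u.reg .rbx = rbx) (h_rsp : u.reg .rsp = rsp) (h_rbp : u.reg .rbp = rbp) (h_rsi : u.reg .rsi = rsi) (h_rdi : u.reg .rdi = rdi) (h_r8 : u.reg .r8 = r8) (h_r9 : u.reg .r9 = r9) (h_r10 : u.reg .r10 = r10) (h_r11 : u.reg .r11 = r11) (h_r12 : u.reg .r12 = r12) (h_r13 : u.reg .r13 = r13) (h_r14 : u.reg .r14 = r14) (h_r15 : u.reg .r15 = r15) (h_rip : u.rip = 0x100000) (h_fl : u.flags = fl) (hμ : μ.vendor = .intel)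
    (hHas : ∀ a n, L.Has a n) (hCan : ∀ a : Word, a < 0x40000000)
    (hNF : ∀ {α : Type} (x : Option α), x ≠ none) (hfam : μ.cfg.field Feature.familyId = 6) (hQ : ∀ v, Q v) :
    InsnGoal L μ u Q (insn% [0xf3, 0x0f, 0x1e, 0xfa]) := by
  u_insn [h_rax, h_rcx, h_rdx, h_rbx, h_rsp, h_rbp, h_rsi, h_rdi, h_r8, h_r9, h_r10, h_r11, h_r12, h_r13, h_r14, h_r15, h_rip, h_fl, hμ]
  all_goals first | exact hHas _ _ | exact hCan _ | exact hNF _ hopt1 | exact Or.inl hfam | exact hQ _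

/-- `bsr eax, ecx` -/
example (h_rax : u.reg .rax = rax) (h_rcx : u.reg .rcx = rcx) (h_rdx : u.reg .rdx = rdx) (h_rbx : u.reg .rbx = rbx) (h_rsp : u.reg .rsp = rsp) (h_rbp : u.reg .rbp = rbp) (h_rsi : u.reg .rsi = rsi) (h_rdi : u.reg .rdi = rdi) (h_r8 : u.reg .r8 = r8) (h_r9 : u.reg .r9 = r9) (h_r10 : u.reg .r10 = r10) (h_r11 : u.reg .r11 = r11) (h_r12 : u.reg .r12 = r12) (h_r13 : u.reg .r13 = r13) (h_r14 : u.reg .r14 = r14) (h_r15 : u.reg .r15 = r15) (h_rip : u.rip = 0x100000) (h_fl : u.flags = fl) (hμ : μ.vendor = .intel)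
    (hHas : ∀ a n, L.Has a n) (hCan : ∀ a : Word, a < 0x40000000)
    (hNF : ∀ {α : Type} (x : Option α), x ≠ none) (hfam : μ.cfg.field Feature.familyId = 6) (hQ : ∀ v, Q v) :
    InsnGoal L μ u Q (insn% [0x0f, 0xbd, 0xc1]) := by
  u_insn [h_rax, h_rcx, h_rdx, h_rbx, h_rsp, h_rbp, h_rsi, h_rdi, h_r8, h_r9, h_r10, h_r11, h_r12, h_r13, h_r14, h_r15, h_rip, h_fl, hμ]
  all_goals first | exact hHas _ _ | exact hCan _ | exact hNF _ hopt1 | exact Or.inl hfam | exact hQ _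

/-- `bsf rax, rcx` -/
example (h_rax : u.reg .rax = rax) (h_rcx : u.reg .rcx = rcx) (h_rdx : u.reg .rdx = rdx) (h_rbx : u.reg .rbx = rbx) (h_rsp : u.reg .rsp = rsp) (h_rbp : u.reg .rbp = rbp) (h_rsi : u.reg .rsi = rsi) (h_rdi : u.reg .rdi = rdi) (h_r8 : u.reg .r8 = r8) (h_r9 : u.reg .r9 = r9) (h_r10 : u.reg .r10 = r10) (h_r11 : u.reg .r11 = r11) (h_r12 : u.reg .r12 = r12) (h_r13 : u.reg .r13 = r13) (h_r14 : u.reg .r14 = r14) (h_r15 : u.reg .r15 = r15) (h_rip : u.rip = 0x100000) (h_fl : u.flags = fl) (hμ : μ.vendor = .intel)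
    (hHas : ∀ a n, L.Has a n) (hCan : ∀ a : Word, a < 0x40000000)
    (hNF : ∀ {α : Type} (x : Option α), x ≠ none) (hfam : μ.cfg.field Feature.familyId = 6) (hQ : ∀ v, Q v) :
    InsnGoal L μ u Q (insn% [0x48, 0x0f, 0xbc, 0xc1]) := by
  u_insn [h_rax, h_rcx, h_rdx, h_rbx, h_rsp, h_rbp, h_rsi, h_rdi, h_r8, h_r9, h_r10, h_r11, h_r12, h_r13, h_r14, h_r15, h_rip, h_fl, hμ]
  all_goals first | exact hHas _ _ | exact hCan _ | exact hNF _ hopt1 | exact Or.inl hfam | exact hQ _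

/-- `xchg rax, rbx` -/
example (h_rax : u.reg .rax = rax) (h_rcx : u.reg .rcx = rcx) (h_rdx : u.reg .rdx = rdx) (h_rbx : u.reg .rbx = rbx) (h_rsp : u.reg .rsp = rsp) (h_rbp : u.reg .rbp = rbp) (h_rsi : u.reg .rsi = rsi) (h_rdi : u.reg .rdi = rdi) (h_r8 : u.reg .r8 = r8) (h_r9 : u.reg .r9 = r9) (h_r10 : u.reg .r10 = r10) (h_r11 : u.reg .r11 = r11) (h_r12 : u.reg .r12 = r12) (h_r13 : u.reg .r13 = r13) (h_r14 : u.reg .r14 = r14) (h_r15 : u.reg .r15 = r15) (h_rip : u.rip = 0x100000) (h_fl : u.flags = fl) (hμ : μ.vendor = .intel)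
    (hHas : ∀ a n, L.Has a n) (hCan : ∀ a : Word, a < 0x40000000)
    (hNF : ∀ {α : Type} (x : Option α), x ≠ none) (hfam : μ.cfg.field Feature.familyId = 6) (hQ : ∀ v, Q v) :
    InsnGoal L μ u Q (insn% [0x48, 0x93]) := by
  u_insn [h_rax, h_rcx, h_rdx, h_rbx, h_rsp, h_rbp, h_rsi, h_rdi, h_r8, h_r9, h_r10, h_r11, h_r12, h_r13, h_r14, h_r15, h_rip, h_fl, hμ]
  all_goals first | exact hHas _ _ | exact hCan _ | exact hNF _ hopt1 | exact Or.inl hfam | exact hQ _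

/-- `cmpxchg ecx, edx` -/
example (h_rax : u.reg .rax = rax) (h_rcx : u.reg .rcx = rcx) (h_rdx : u.reg .rdx = rdx) (h_rbx : u.reg .rbx = rbx) (h_rsp : u.reg .rsp = rsp) (h_rbp : u.reg .rbp = rbp) (h_rsi : u.reg .rsi = rsi) (h_rdi : u.reg .rdi = rdi) (h_r8 : u.reg .r8 = r8) (h_r9 : u.reg .r9 = r9) (h_r10 : u.reg .r10 = r10) (h_r11 : u.reg .r11 = r11) (h_r12 : u.reg .r12 = r12) (h_r13 : u.reg .r13 = r13) (h_r14 : u.reg .r14 = r14) (h_r15 : u.reg .r15 = r15) (h_rip : u.rip = 0x100000) (h_fl : u.flags = fl) (hμ : μ.vendor = .intel)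
    (hHas : ∀ a n, L.Has a n) (hCan : ∀ a : Word, a < 0x40000000)
    (hNF : ∀ {α : Type} (x : Option α), x ≠ none) (hfam : μ.cfg.field Feature.familyId = 6) (hQ : ∀ v, Q v) :
    InsnGoal L μ u Q (insn% [0x0f, 0xb1, 0xd1]) := by
  u_insn [h_rax, h_rcx, h_rdx, h_rbx, h_rsp, h_rbp, h_rsi, h_rdi, h_r8, h_r9, h_r10, h_r11, h_r12, h_r13, h_r14, h_r15, h_rip, h_fl, hμ]
  all_goals first | exact hHas _ _ | exact hCan _ | exact hNF _ hopt1 | exact Or.inl hfam | exact hQ _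

/-- `bt eax, 0x3` -/
example (h_rax : u.reg .rax = rax) (h_rcx : u.reg .rcx = rcx) (h_rdx : u.reg .rdx = rdx) (h_rbx : u.reg .rbx = rbx) (h_rsp : u.reg .rsp = rsp) (h_rbp : u.reg .rbp = rbp) (h_rsi : u.reg .rsi = rsi) (h_rdi : u.reg .rdi = rdi) (h_r8 : u.reg .r8 = r8) (h_r9 : u.reg .r9 = r9) (h_r10 : u.reg .r10 = r10) (h_r11 : u.reg .r11 = r11) (h_r12 : u.reg .r12 = r12) (h_r13 : u.reg .r13 = r13) (h_r14 : u.reg .r14 = r14) (h_r15 : u.reg .r15 = r15) (h_rip : u.rip = 0x100000) (h_fl : u.flags = fl) (hμ : μ.vendor = .intel)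
    (hHas : ∀ a n, L.Has a n) (hCan : ∀ a : Word, a < 0x40000000)
    (hNF : ∀ {α : Type} (x : Option α), x ≠ none) (hfam : μ.cfg.field Feature.familyId = 6) (hQ : ∀ v, Q v) :
    InsnGoal L μ u Q (insn% [0x0f, 0xba, 0xe0, 0x03]) := by
  u_insn [h_rax, h_rcx, h_rdx, h_rbx, h_rsp, h_rbp, h_rsi, h_rdi, h_r8, h_r9, h_r10, h_r11, h_r12, h_r13, h_r14, h_r15, h_rip, h_fl, hμ]
  all_goals first | exact hHas _ _ | exact hCan _ | exact hNF _ hopt1 | exact Or.inl hfam | exact hQ _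

/-- `cld` -/
example (h_rax : u.reg .rax = rax) (h_rcx : u.reg .rcx = rcx) (h_rdx : u.reg .rdx = rdx) (h_rbx : u.reg .rbx = rbx) (h_rsp : u.reg .rsp = rsp) (h_rbp : u.reg .rbp = rbp) (h_rsi : u.reg .rsi = rsi) (h_rdi : u.reg .rdi = rdi) (h_r8 : u.reg .r8 = r8) (h_r9 : u.reg .r9 = r9) (h_r10 : u.reg .r10 = r10) (h_r11 : u.reg .r11 = r11) (h_r12 : u.reg .r12 = r12) (h_r13 : u.reg .r13 = r13) (h_r14 : u.reg .r14 = r14) (h_r15 : u.reg .r15 = r15) (h_rip : u.rip = 0x100000) (h_fl : u.flags = fl) (hμ : μ.vendor = .intel)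
    (hHas : ∀ a n, L.Has a n) (hCan : ∀ a : Word, a < 0x40000000)
    (hNF : ∀ {α : Type} (x : Option α), x ≠ none) (hfam : μ.cfg.field Feature.familyId = 6) (hQ : ∀ v, Q v) :
    InsnGoal L μ u Q (insn% [0xfc]) := by
  u_insn [h_rax, h_rcx, h_rdx, h_rbx, h_rsp, h_rbp, h_rsi, h_rdi, h_r8, h_r9, h_r10, h_r11, h_r12, h_r13, h_r14, h_r15, h_rip, h_fl, hμ]
  all_goals first | exact hHas _ _ | exact hCan _ | exact hNF _ hopt1 | exact Or.inl hfam | exact hQ _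

/-- `hex:e8a17a0000` -/
example (h_rax : u.reg .rax = rax) (h_rcx : u.reg .rcx = rcx) (h_rdx : u.reg .rdx = rdx) (h_rbx : u.reg .rbx = rbx) (h_rsp : u.reg .rsp = rsp) (h_rbp : u.reg .rbp = rbp) (h_rsi : u.reg .rsi = rsi) (h_rdi : u.reg .rdi = rdi) (h_r8 : u.reg .r8 = r8) (h_r9 : u.reg .r9 = r9) (h_r10 : u.reg .r10 = r10) (h_r11 : u.reg .r11 = r11) (h_r12 : u.reg .r12 = r12) (h_r13 : u.reg .r13 = r13) (h_r14 : u.reg .r14 = r14) (h_r15 : u.reg .r15 = r15) (h_rip : u.rip = 0x100000) (h_fl : u.flags = fl) (hμ : μ.vendor = .intel)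
    (hHas : ∀ a n, L.Has a n) (hCan : ∀ a : Word, a < 0x40000000)
    (hNF : ∀ {α : Type} (x : Option α), x ≠ none) (hfam : μ.cfg.field Feature.familyId = 6) (hQ : ∀ v, Q v) :
    InsnGoal L μ u Q (insn% [0xe8, 0xa1, 0x7a, 0x00, 0x00]) := by
  u_insn [h_rax, h_rcx, h_rdx, h_rbx, h_rsp, h_rbp, h_rsi, h_rdi, h_r8, h_r9, h_r10, h_r11, h_r12, h_r13, h_r14, h_r15, h_rip, h_fl, hμ]
  all_goals first | exact hHas _ _ | exact hCan _ | exact hNF _ hopt1 | exact Or.inl hfam | exact hQ _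

/-- `hex:44896d00` -/
example (h_rax : u.reg .rax = rax) (h_rcx : u.reg .rcx = rcx) (h_rdx : u.reg .rdx = rdx) (h_rbx : u.reg .rbx = rbx) (h_rsp : u.reg .rsp = rsp) (h_rbp : u.reg .rbp = rbp) (h_rsi : u.reg .rsi = rsi) (h_rdi : u.reg .rdi = rdi) (h_r8 : u.reg .r8 = r8) (h_r9 : u.reg .r9 = r9) (h_r10 : u.reg .r10 = r10) (h_r11 : u.reg .r11 = r11) (h_r12 : u.reg .r12 = r12) (h_r13 : u.reg .r13 = r13) (h_r14 : u.reg .r14 = r14) (h_r15 : u.reg .r15 = r15) (h_rip : u.rip = 0x100000) (h_fl : u.flags = fl) (hμ : μ.vendor = .intel)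
    (hHas : ∀ a n, L.Has a n) (hCan : ∀ a : Word, a < 0x40000000)
    (hNF : ∀ {α : Type} (x : Option α), x ≠ none) (hfam : μ.cfg.field Feature.familyId = 6) (hQ : ∀ v, Q v) :
    InsnGoal L μ u Q (insn% [0x44, 0x89, 0x6d, 0x00]) := by
  u_insn [h_rax, h_rcx, h_rdx, h_rbx, h_rsp, h_rbp, h_rsi, h_rdi, h_r8, h_r9, h_r10, h_r11, h_r12, h_r13, h_r14, h_r15, h_rip, h_fl, hμ]
  all_goals first | exact hHas _ _ | exact hCan _ | exact hNF _ hopt1 | exact Or.inl hfam | exact hQ _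

/-- `hex:498d7e10` -/
example (h_rax : u.reg .rax = rax) (h_rcx : u.reg .rcx = rcx) (h_rdx : u.reg .rdx = rdx) (h_rbx : u.reg .rbx = rbx) (h_rsp : u.reg .rsp = rsp) (h_rbp : u.reg .rbp = rbp) (h_rsi : u.reg .rsi = rsi) (h_rdi : u.reg .rdi = rdi) (h_r8 : u.reg .r8 = r8) (h_r9 : u.reg .r9 = r9) (h_r10 : u.reg .r10 = r10) (h_r11 : u.reg .r11 = r11) (h_r12 : u.reg .r12 = r12) (h_r13 : u.reg .r13 = r13) (h_r14 : u.reg .r14 = r14) (h_r15 : u.reg .r15 = r15) (h_rip : u.rip = 0x100000) (h_fl : u.flags = fl) (hμ : μ.vendor = .intel)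
    (hHas : ∀ a n, L.Has a n) (hCan : ∀ a : Word, a < 0x40000000)
    (hNF : ∀ {α : Type} (x : Option α), x ≠ none) (hfam : μ.cfg.field Feature.familyId = 6) (hQ : ∀ v, Q v) :
    InsnGoal L μ u Q (insn% [0x49, 0x8d, 0x7e, 0x10]) := by
  u_insn [h_rax, h_rcx, h_rdx, h_rbx, h_rsp, h_rbp, h_rsi, h_rdi, h_r8, h_r9, h_r10, h_r11, h_r12, h_r13, h_r14, h_r15, h_rip, h_fl, hμ]
  all_goals first | exact hHas _ _ | exact hCan _ | exact hNF _ hopt1 | exact Or.inl hfam | exact hQ _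

/-- `hex:7d5b` -/
example (h_rax : u.reg .rax = rax) (h_rcx : u.reg .rcx = rcx) (h_rdx : u.reg .rdx = rdx) (h_rbx : u.reg .rbx = rbx) (h_rsp : u.reg .rsp = rsp) (h_rbp : u.reg .rbp = rbp) (h_rsi : u.reg .rsi = rsi) (h_rdi : u.reg .rdi = rdi) (h_r8 : u.reg .r8 = r8) (h_r9 : u.reg .r9 = r9) (h_r10 : u.reg .r10 = r10) (h_r11 : u.reg .r11 = r11) (h_r12 : u.reg .r12 = r12) (h_r13 : u.reg .r13 = r13) (h_r14 : u.reg .r14 = r14) (h_r15 : u.reg .r15 = r15) (h_rip : u.rip = 0x100000) (h_fl : u.flags = fl) (hμ : μ.vendor = .intel)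
    (hHas : ∀ a n, L.Has a n) (hCan : ∀ a : Word, a < 0x40000000)
    (hNF : ∀ {α : Type} (x : Option α), x ≠ none) (hfam : μ.cfg.field Feature.familyId = 6) (hQ : ∀ v, Q v) :
    InsnGoal L μ u Q (insn% [0x7d, 0x5b]) := by
  u_insn [h_rax, h_rcx, h_rdx, h_rbx, h_rsp, h_rbp, h_rsi, h_rdi, h_r8, h_r9, h_r10, h_r11, h_r12, h_r13, h_r14, h_r15, h_rip, h_fl, hμ]
  all_goals first | exact hHas _ _ | exact hCan _ | exact hNF _ hopt1 | exact Or.inl hfam | exact hQ _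

/-- `hex:e93cd3ffff` -/
example (h_rax : u.reg .rax = rax) (h_rcx : u.reg .rcx = rcx) (h_rdx : u.reg .rdx = rdx) (h_rbx : u.reg .rbx = rbx) (h_rsp : u.reg .rsp = rsp) (h_rbp : u.reg .rbp = rbp) (h_rsi : u.reg .rsi = rsi) (h_rdi : u.reg .rdi = rdi) (h_r8 : u.reg .r8 = r8) (h_r9 : u.reg .r9 = r9) (h_r10 : u.reg .r10 = r10) (h_r11 : u.reg .r11 = r11) (h_r12 : u.reg .r12 = r12) (h_r13 : u.reg .r13 = r13) (h_r14 : u.reg .r14 = r14) (h_r15 : u.reg .r15 = r15) (h_rip : u.rip = 0x100000) (h_fl : u.flags = fl) (hμ : μ.vendor = .intel)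
    (hHas : ∀ a n, L.Has a n) (hCan : ∀ a : Word, a < 0x40000000)
    (hNF : ∀ {α : Type} (x : Option α), x ≠ none) (hfam : μ.cfg.field Feature.familyId = 6) (hQ : ∀ v, Q v) :
    InsnGoal L μ u Q (insn% [0xe9, 0x3c, 0xd3, 0xff, 0xff]) := by
  u_insn [h_rax, h_rcx, h_rdx, h_rbx, h_rsp, h_rbp, h_rsi, h_rdi, h_r8, h_r9, h_r10, h_r11, h_r12, h_r13, h_r14, h_r15, h_rip, h_fl, hμ]
  all_goals first | exact hHas _ _ | exact hCan _ | exact hNF _ hopt1 | exact Or.inl hfam | exact hQ _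

/-- `hex:4839c3` -/
example (h_rax : u.reg .rax = rax) (h_rcx : u.reg .rcx = rcx) (h_rdx : u.reg .rdx = rdx) (h_rbx : u.reg .rbx = rbx) (h_rsp : u.reg .rsp = rsp) (h_rbp : u.reg .rbp = rbp) (h_rsi : u.reg .rsi = rsi) (h_rdi : u.reg .rdi = rdi) (h_r8 : u.reg .r8 = r8) (h_r9 : u.reg .r9 = r9) (h_r10 : u.reg .r10 = r10) (h_r11 : u.reg .r11 = r11) (h_r12 : u.reg .r12 = r12) (h_r13 : u.reg .r13 = r13) (h_r14 : u.reg .r14 = r14) (h_r15 : u.reg .r15 = r15) (h_rip : u.rip = 0x100000) (h_fl : u.flags = fl) (hμ : μ.vendor = .intel)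
    (hHas : ∀ a n, L.Has a n) (hCan : ∀ a : Word, a < 0x40000000)
    (hNF : ∀ {α : Type} (x : Option α), x ≠ none) (hfam : μ.cfg.field Feature.familyId = 6) (hQ : ∀ v, Q v) :
    InsnGoal L μ u Q (insn% [0x48, 0x39, 0xc3]) := by
  u_insn [h_rax, h_rcx, h_rdx, h_rbx, h_rsp, h_rbp, h_rsi, h_rdi, h_r8, h_r9, h_r10, h_r11, h_r12, h_r13, h_r14, h_r15, h_rip, h_fl, hμ]
  all_goals first | exact hHas _ _ | exact hCan _ | exact hNF _ hopt1 | exact Or.inl hfam | exact hQ _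

/-- `hex:4c036b28` -/
example (h_rax : u.reg .rax = rax) (h_rcx : u.reg .rcx = rcx) (h_rdx : u.reg .rdx = rdx) (h_rbx : u.reg .rbx = rbx) (h_rsp : u.reg .rsp = rsp) (h_rbp : u.reg .rbp = rbp) (h_rsi : u.reg .rsi = rsi) (h_rdi : u.reg .rdi = rdi) (h_r8 : u.reg .r8 = r8) (h_r9 : u.reg .r9 = r9) (h_r10 : u.reg .r10 = r10) (h_r11 : u.reg .r11 = r11) (h_r12 : u.reg .r12 = r12) (h_r13 : u.reg .r13 = r13) (h_r14 : u.reg .r14 = r14) (h_r15 : u.reg .r15 = r15) (h_rip : u.rip = 0x100000) (h_fl : u.flags = fl) (hμ : μ.vendor = .intel)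
    (hHas : ∀ a n, L.Has a n) (hCan : ∀ a : Word, a < 0x40000000)
    (hNF : ∀ {α : Type} (x : Option α), x ≠ none) (hfam : μ.cfg.field Feature.familyId = 6) (hQ : ∀ v, Q v) :
    InsnGoal L μ u Q (insn% [0x4c, 0x03, 0x6b, 0x28]) := by
  u_insn [h_rax, h_rcx, h_rdx, h_rbx, h_rsp, h_rbp, h_rsi, h_rdi, h_r8, h_r9, h_r10, h_r11, h_r12, h_r13, h_r14, h_r15, h_rip, h_fl, hμ]
  all_goals first | exact hHas _ _ | exact hCan _ | exact hNF _ hopt1 | exact Or.inl hfam | exact hQ _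

/-- `hex:410fb67618` -/
example (h_rax : u.reg .rax = rax) (h_rcx : u.reg .rcx = rcx) (h_rdx : u.reg .rdx = rdx) (h_rbx : u.reg .rbx = rbx) (h_rsp : u.reg .rsp = rsp) (h_rbp : u.reg .rbp = rbp) (h_rsi : u.reg .rsi = rsi) (h_rdi : u.reg .rdi = rdi) (h_r8 : u.reg .r8 = r8) (h_r9 : u.reg .r9 = r9) (h_r10 : u.reg .r10 = r10) (h_r11 : u.reg .r11 = r11) (h_r12 : u.reg .r12 = r12) (h_r13 : u.reg .r13 = r13) (h_r14 : u.reg .r14 = r14) (h_r15 : u.reg .r15 = r15) (h_rip : u.rip = 0x100000) (h_fl : u.flags = fl) (hμ : μ.vendor = .intel)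
    (hHas : ∀ a n, L.Has a n) (hCan : ∀ a : Word, a < 0x40000000)
    (hNF : ∀ {α : Type} (x : Option α), x ≠ none) (hfam : μ.cfg.field Feature.familyId = 6) (hQ : ∀ v, Q v) :
    InsnGoal L μ u Q (insn% [0x41, 0x0f, 0xb6, 0x76, 0x18]) := by
  u_insn [h_rax, h_rcx, h_rdx, h_rbx, h_rsp, h_rbp, h_rsi, h_rdi, h_r8, h_r9, h_r10, h_r11, h_r12, h_r13, h_r14, h_r15, h_rip, h_fl, hμ]
  all_goals first | exact hHas _ _ | exact hCan _ | exact hNF _ hopt1 | exact Or.inl hfam | exact hQ _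

/-- `hex:4d63fe` -/
example (h_rax : u.reg .rax = rax) (h_rcx : u.reg .rcx = rcx) (h_rdx : u.reg .rdx = rdx) (h_rbx : u.reg .rbx = rbx) (h_rsp : u.reg .rsp = rsp) (h_rbp : u.reg .rbp = rbp) (h_rsi : u.reg .rsi = rsi) (h_rdi : u.reg .rdi = rdi) (h_r8 : u.reg .r8 = r8) (h_r9 : u.reg .r9 = r9) (h_r10 : u.reg .r10 = r10) (h_r11 : u.reg .r11 = r11) (h_r12 : u.reg .r12 = r12) (h_r13 : u.reg .r13 = r13) (h_r14 : u.reg .r14 = r14) (h_r15 : u.reg .r15 = r15) (h_rip : u.rip = 0x100000) (h_fl : u.flags = fl) (hμ : μ.vendor = .intel)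
    (hHas : ∀ a n, L.Has a n) (hCan : ∀ a : Word, a < 0x40000000)
    (hNF : ∀ {α : Type} (x : Option α), x ≠ none) (hfam : μ.cfg.field Feature.familyId = 6) (hQ : ∀ v, Q v) :
    InsnGoal L μ u Q (insn% [0x4d, 0x63, 0xfe]) := by
  u_insn [h_rax, h_rcx, h_rdx, h_rbx, h_rsp, h_rbp, h_rsi, h_rdi, h_r8, h_r9, h_r10, h_r11, h_r12, h_r13, h_r14, h_r15, h_rip, h_fl, hμ]
  all_goals first | exact hHas _ _ | exact hCan _ | exact hNF _ hopt1 | exact Or.inl hfam | exact hQ _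

/-- `hex:29f0` -/
example (h_rax : u.reg .rax = rax) (h_rcx : u.reg .rcx = rcx) (h_rdx : u.reg .rdx = rdx) (h_rbx : u.reg .rbx = rbx) (h_rsp : u.reg .rsp = rsp) (h_rbp : u.reg .rbp = rbp) (h_rsi : u.reg .rsi = rsi) (h_rdi : u.reg .rdi = rdi) (h_r8 : u.reg .r8 = r8) (h_r9 : u.reg .r9 = r9) (h_r10 : u.reg .r10 = r10) (h_r11 : u.reg .r11 = r11) (h_r12 : u.reg .r12 = r12) (h_r13 : u.reg .r13 = r13) (h_r14 : u.reg .r14 = r14) (h_r15 : u.reg .r15 = r15) (h_rip : u.rip = 0x100000) (h_fl : u.flags = fl) (hμ : μ.vendor = .intel)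
    (hHas : ∀ a n, L.Has a n) (hCan : ∀ a : Word, a < 0x40000000)
    (hNF : ∀ {α : Type} (x : Option α), x ≠ none) (hfam : μ.cfg.field Feature.familyId = 6) (hQ : ∀ v, Q v) :
    InsnGoal L μ u Q (insn% [0x29, 0xf0]) := by
  u_insn [h_rax, h_rcx, h_rdx, h_rbx, h_rsp, h_rbp, h_rsi, h_rdi, h_r8, h_r9, h_r10, h_r11, h_r12, h_r13, h_r14, h_r15, h_rip, h_fl, hμ]
  all_goals first | exact hHas _ _ | exact hCan _ | exact hNF _ hopt1 | exact Or.inl hfam | exact hQ _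

/-- `hex:48c1e004` -/
example (h_rax : u.reg .rax = rax) (h_rcx : u.reg .rcx = rcx) (h_rdx : u.reg .rdx = rdx) (h_rbx : u.reg .rbx = rbx) (h_rsp : u.reg .rsp = rsp) (h_rbp : u.reg .rbp = rbp) (h_rsi : u.reg .rsi = rsi) (h_rdi : u.reg .rdi = rdi) (h_r8 : u.reg .r8 = r8) (h_r9 : u.reg .r9 = r9) (h_r10 : u.reg .r10 = r10) (h_r11 : u.reg .r11 = r11) (h_r12 : u.reg .r12 = r12) (h_r13 : u.reg .r13 = r13) (h_r14 : u.reg .r14 = r14) (h_r15 : u.reg .r15 = r15) (h_rip : u.rip = 0x100000) (h_fl : u.flags = fl) (hμ : μ.vendor = .intel)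
    (hHas : ∀ a n, L.Has a n) (hCan : ∀ a : Word, a < 0x40000000)
    (hNF : ∀ {α : Type} (x : Option α), x ≠ none) (hfam : μ.cfg.field Feature.familyId = 6) (hQ : ∀ v, Q v) :
    InsnGoal L μ u Q (insn% [0x48, 0xc1, 0xe0, 0x04]) := by
  u_insn [h_rax, h_rcx, h_rdx, h_rbx, h_rsp, h_rbp, h_rsi, h_rdi, h_r8, h_r9, h_r10, h_r11, h_r12, h_r13, h_r14, h_r15, h_rip, h_fl, hμ]
  all_goals first | exact hHas _ _ | exact hCan _ | exact hNF _ hopt1 | exact Or.inl hfam | exact hQ _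

/-- `hex:66f7c30080` -/
example (h_rax : u.reg .rax = rax) (h_rcx : u.reg .rcx = rcx) (h_rdx : u.reg .rdx = rdx) (h_rbx : u.reg .rbx = rbx) (h_rsp : u.reg .rsp = rsp) (h_rbp : u.reg .rbp = rbp) (h_rsi : u.reg .rsi = rsi) (h_rdi : u.reg .rdi = rdi) (h_r8 : u.reg .r8 = r8) (h_r9 : u.reg .r9 = r9) (h_r10 : u.reg .r10 = r10) (h_r11 : u.reg .r11 = r11) (h_r12 : u.reg .r12 = r12) (h_r13 : u.reg .r13 = r13) (h_r14 : u.reg .r14 = r14) (h_r15 : u.reg .r15 = r15) (h_rip : u.rip = 0x100000) (h_fl : u.flags = fl) (hμ : μ.vendor = .intel)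
    (hHas : ∀ a n, L.Has a n) (hCan : ∀ a : Word, a < 0x40000000)
    (hNF : ∀ {α : Type} (x : Option α), x ≠ none) (hfam : μ.cfg.field Feature.familyId = 6) (hQ : ∀ v, Q v) :
    InsnGoal L μ u Q (insn% [0x66, 0xf7, 0xc3, 0x00, 0x80]) := by
  u_insn [h_rax, h_rcx, h_rdx, h_rbx, h_rsp, h_rbp, h_rsi, h_rdi, h_r8, h_r9, h_r10, h_r11, h_r12, h_r13, h_r14, h_r15, h_rip, h_fl, hμ]
  all_goals first | exact hHas _ _ | exact hCan _ | exact hNF _ hopt1 | exact Or.inl hfam | exact hQ _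

/-- `hex:41c1fc02` -/
example (h_rax : u.reg .rax = rax) (h_rcx : u.reg .rcx = rcx) (h_rdx : u.reg .rdx = rdx) (h_rbx : u.reg .rbx = rbx) (h_rsp : u.reg .rsp = rsp) (h_rbp : u.reg .rbp = rbp) (h_rsi : u.reg .rsi = rsi) (h_rdi : u.reg .rdi = rdi) (h_r8 : u.reg .r8 = r8) (h_r9 : u.reg .r9 = r9) (h_r10 : u.reg .r10 = r10) (h_r11 : u.reg .r11 = r11) (h_r12 : u.reg .r12 = r12) (h_r13 : u.reg .r13 = r13) (h_r14 : u.reg .r14 = r14) (h_r15 : u.reg .r15 = r15) (h_rip : u.rip = 0x100000) (h_fl : u.flags = fl) (hμ : μ.vendor = .intel)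
    (hHas : ∀ a n, L.Has a n) (hCan : ∀ a : Word, a < 0x40000000)
    (hNF : ∀ {α : Type} (x : Option α), x ≠ none) (hfam : μ.cfg.field Feature.familyId = 6) (hQ : ∀ v, Q v) :
    InsnGoal L μ u Q (insn% [0x41, 0xc1, 0xfc, 0x02]) := by
  u_insn [h_rax, h_rcx, h_rdx, h_rbx, h_rsp, h_rbp, h_rsi, h_rdi, h_r8, h_r9, h_r10, h_r11, h_r12, h_r13, h_r14, h_r15, h_rip, h_fl, hμ]
  all_goals first | exact hHas _ _ | exact hCan _ | exact hNF _ hopt1 | exact Or.inl hfam | exact hQ _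

/-- `hex:83e207` -/
example (h_rax : u.reg .rax = rax) (h_rcx : u.reg .rcx = rcx) (h_rdx : u.reg .rdx = rdx) (h_rbx : u.reg .rbx = rbx) (h_rsp : u.reg .rsp = rsp) (h_rbp : u.reg .rbp = rbp) (h_rsi : u.reg .rsi = rsi) (h_rdi : u.reg .rdi = rdi) (h_r8 : u.reg .r8 = r8) (h_r9 : u.reg .r9 = r9) (h_r10 : u.reg .r10 = r10) (h_r11 : u.reg .r11 = r11) (h_r12 : u.reg .r12 = r12) (h_r13 : u.reg .r13 = r13) (h_r14 : u.reg .r14 = r14) (h_r15 : u.reg .r15 = r15) (h_rip : u.rip = 0x100000) (h_fl : u.flags = fl) (hμ : μ.vendor = .intel)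
    (hHas : ∀ a n, L.Has a n) (hCan : ∀ a : Word, a < 0x40000000)
    (hNF : ∀ {α : Type} (x : Option α), x ≠ none) (hfam : μ.cfg.field Feature.familyId = 6) (hQ : ∀ v, Q v) :
    InsnGoal L μ u Q (insn% [0x83, 0xe2, 0x07]) := by
  u_insn [h_rax, h_rcx, h_rdx, h_rbx, h_rsp, h_rbp, h_rsi, h_rdi, h_r8, h_r9, h_r10, h_r11, h_r12, h_r13, h_r14, h_r15, h_rip, h_fl, hμ]
  all_goals first | exact hHas _ _ | exact hCan _ | exact hNF _ hopt1 | exact Or.inl hfam | exact hQ _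

/-- `hex:410faffd` -/
example (h_rax : u.reg .rax = rax) (h_rcx : u.reg .rcx = rcx) (h_rdx : u.reg .rdx = rdx) (h_rbx : u.reg .rbx = rbx) (h_rsp : u.reg .rsp = rsp) (h_rbp : u.reg .rbp = rbp) (h_rsi : u.reg .rsi = rsi) (h_rdi : u.reg .rdi = rdi) (h_r8 : u.reg .r8 = r8) (h_r9 : u.reg .r9 = r9) (h_r10 : u.reg .r10 = r10) (h_r11 : u.reg .r11 = r11) (h_r12 : u.reg .r12 = r12) (h_r13 : u.reg .r13 = r13) (h_r14 : u.reg .r14 = r14) (h_r15 : u.reg .r15 = r15) (h_rip : u.rip = 0x100000) (h_fl : u.flags = fl) (hμ : μ.vendor = .intel)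
    (hHas : ∀ a n, L.Has a n) (hCan : ∀ a : Word, a < 0x40000000)
    (hNF : ∀ {α : Type} (x : Option α), x ≠ none) (hfam : μ.cfg.field Feature.familyId = 6) (hQ : ∀ v, Q v) :
    InsnGoal L μ u Q (insn% [0x41, 0x0f, 0xaf, 0xfd]) := by
  u_insn [h_rax, h_rcx, h_rdx, h_rbx, h_rsp, h_rbp, h_rsi, h_rdi, h_r8, h_r9, h_r10, h_r11, h_r12, h_r13, h_r14, h_r15, h_rip, h_fl, hμ]
  all_goals first | exact hHas _ _ | exact hCan _ | exact hNF _ hopt1 | exact Or.inl hfam | exact hQ _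

/-- `hex:48c1e834` -/
example (h_rax : u.reg .rax = rax) (h_rcx : u.reg .rcx = rcx) (h_rdx : u.reg .rdx = rdx) (h_rbx : u.reg .rbx = rbx) (h_rsp : u.reg .rsp = rsp) (h_rbp : u.reg .rbp = rbp) (h_rsi : u.reg .rsi = rsi) (h_rdi : u.reg .rdi = rdi) (h_r8 : u.reg .r8 = r8) (h_r9 : u.reg .r9 = r9) (h_r10 : u.reg .r10 = r10) (h_r11 : u.reg .r11 = r11) (h_r12 : u.reg .r12 = r12) (h_r13 : u.reg .r13 = r13) (h_r14 : u.reg .r14 = r14) (h_r15 : u.reg .r15 = r15) (h_rip : u.rip = 0x100000) (h_fl : u.flags = fl) (hμ : μ.vendor = .intel)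
    (hHas : ∀ a n, L.Has a n) (hCan : ∀ a : Word, a < 0x40000000)
    (hNF : ∀ {α : Type} (x : Option α), x ≠ none) (hfam : μ.cfg.field Feature.familyId = 6) (hQ : ∀ v, Q v) :
    InsnGoal L μ u Q (insn% [0x48, 0xc1, 0xe8, 0x34]) := by
  u_insn [h_rax, h_rcx, h_rdx, h_rbx, h_rsp, h_rbp, h_rsi, h_rdi, h_r8, h_r9, h_r10, h_r11, h_r12, h_r13, h_r14, h_r15, h_rip, h_fl, hμ]
  all_goals first | exact hHas _ _ | exact hCan _ | exact hNF _ hopt1 | exact Or.inl hfam | exact hQ _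

/-- `hex:416bf530` -/
example (h_rax : u.reg .rax = rax) (h_rcx : u.reg .rcx = rcx) (h_rdx : u.reg .rdx = rdx) (h_rbx : u.reg .rbx = rbx) (h_rsp : u.reg .rsp = rsp) (h_rbp : u.reg .rbp = rbp) (h_rsi : u.reg .rsi = rsi) (h_rdi : u.reg .rdi = rdi) (h_r8 : u.reg .r8 = r8) (h_r9 : u.reg .r9 = r9) (h_r10 : u.reg .r10 = r10) (h_r11 : u.reg .r11 = r11) (h_r12 : u.reg .r12 = r12) (h_r13 : u.reg .r13 = r13) (h_r14 : u.reg .r14 = r14) (h_r15 : u.reg .r15 = r15) (h_rip : u.rip = 0x100000) (h_fl : u.flags = fl) (hμ : μ.vendor = .intel)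
    (hHas : ∀ a n, L.Has a n) (hCan : ∀ a : Word, a < 0x40000000)
    (hNF : ∀ {α : Type} (x : Option α), x ≠ none) (hfam : μ.cfg.field Feature.familyId = 6) (hQ : ∀ v, Q v) :
    InsnGoal L μ u Q (insn% [0x41, 0x6b, 0xf5, 0x30]) := by
  u_insn [h_rax, h_rcx, h_rdx, h_rbx, h_rsp, h_rbp, h_rsi, h_rdi, h_r8, h_r9, h_r10, h_r11, h_r12, h_r13, h_r14, h_r15, h_rip, h_fl, hμ]
  all_goals first | exact hHas _ _ | exact hCan _ | exact hNF _ hopt1 | exact Or.inl hfam | exact hQ _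

/-- `hex:0f9ec0` -/
example (h_rax : u.reg .rax = rax) (h_rcx : u.reg .rcx = rcx) (h_rdx : u.reg .rdx = rdx) (h_rbx : u.reg .rbx = rbx) (h_rsp : u.reg .rsp = rsp) (h_rbp : u.reg .rbp = rbp) (h_rsi : u.reg .rsi = rsi) (h_rdi : u.reg .rdi = rdi) (h_r8 : u.reg .r8 = r8) (h_r9 : u.reg .r9 = r9) (h_r10 : u.reg .r10 = r10) (h_r11 : u.reg .r11 = r11) (h_r12 : u.reg .r12 = r12) (h_r13 : u.reg .r13 = r13) (h_r14 : u.reg .r14 = r14) (h_r15 : u.reg .r15 = r15) (h_rip : u.rip = 0x100000) (h_fl : u.flags = fl) (hμ : μ.vendor = .intel)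
    (hHas : ∀ a n, L.Has a n) (hCan : ∀ a : Word, a < 0x40000000)
    (hNF : ∀ {α : Type} (x : Option α), x ≠ none) (hfam : μ.cfg.field Feature.familyId = 6) (hQ : ∀ v, Q v) :
    InsnGoal L μ u Q (insn% [0x0f, 0x9e, 0xc0]) := by
  u_insn [h_rax, h_rcx, h_rdx, h_rbx, h_rsp, h_rbp, h_rsi, h_rdi, h_r8, h_r9, h_r10, h_r11, h_r12, h_r13, h_r14, h_r15, h_rip, h_fl, hμ]
  all_goals first | exact hHas _ _ | exact hCan _ | exact hNF _ hopt1 | exact Or.inl hfam | exact hQ _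

/-- `hex:4157` -/
example (h_rax : u.reg .rax = rax) (h_rcx : u.reg .rcx = rcx) (h_rdx : u.reg .rdx = rdx) (h_rbx : u.reg .rbx = rbx) (h_rsp : u.reg .rsp = rsp) (h_rbp : u.reg .rbp = rbp) (h_rsi : u.reg .rsi = rsi) (h_rdi : u.reg .rdi = rdi) (h_r8 : u.reg .r8 = r8) (h_r9 : u.reg .r9 = r9) (h_r10 : u.reg .r10 = r10) (h_r11 : u.reg .r11 = r11) (h_r12 : u.reg .r12 = r12) (h_r13 : u.reg .r13 = r13) (h_r14 : u.reg .r14 = r14) (h_r15 : u.reg .r15 = r15) (h_rip : u.rip = 0x100000) (h_fl : u.flags = fl) (hμ : μ.vendor = .intel)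
    (hHas : ∀ a n, L.Has a n) (hCan : ∀ a : Word, a < 0x40000000)
    (hNF : ∀ {α : Type} (x : Option α), x ≠ none) (hfam : μ.cfg.field Feature.familyId = 6) (hQ : ∀ v, Q v) :
    InsnGoal L μ u Q (insn% [0x41, 0x57]) := by
  u_insn [h_rax, h_rcx, h_rdx, h_rbx, h_rsp, h_rbp, h_rsi, h_rdi, h_r8, h_r9, h_r10, h_r11, h_r12, h_r13, h_r14, h_r15, h_rip, h_fl, hμ]
  all_goals first | exact hHas _ _ | exact hCan _ | exact hNF _ hopt1 | exact Or.inl hfam | exact hQ _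

/-- `hex:415f` -/
example (h_rax : u.reg .rax = rax) (h_rcx : u.reg .rcx = rcx) (h_rdx : u.reg .rdx = rdx) (h_rbx : u.reg .rbx = rbx) (h_rsp : u.reg .rsp = rsp) (h_rbp : u.reg .rbp = rbp) (h_rsi : u.reg .rsi = rsi) (h_rdi : u.reg .rdi = rdi) (h_r8 : u.reg .r8 = r8) (h_r9 : u.reg .r9 = r9) (h_r10 : u.reg .r10 = r10) (h_r11 : u.reg .r11 = r11) (h_r12 : u.reg .r12 = r12) (h_r13 : u.reg .r13 = r13) (h_r14 : u.reg .r14 = r14) (h_r15 : u.reg .r15 = r15) (h_rip : u.rip = 0x100000) (h_fl : u.flags = fl) (hμ : μ.vendor = .intel)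
    (hHas : ∀ a n, L.Has a n) (hCan : ∀ a : Word, a < 0x40000000)
    (hNF : ∀ {α : Type} (x : Option α), x ≠ none) (hfam : μ.cfg.field Feature.familyId = 6) (hQ : ∀ v, Q v) :
    InsnGoal L μ u Q (insn% [0x41, 0x5f]) := by
  u_insn [h_rax, h_rcx, h_rdx, h_rbx, h_rsp, h_rbp, h_rsi, h_rdi, h_r8, h_r9, h_r10, h_r11, h_r12, h_r13, h_r14, h_r15, h_rip, h_fl, hμ]
  all_goals first | exact hHas _ _ | exact hCan _ | exact hNF _ hopt1 | exact Or.inl hfam | exact hQ _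

/-- `hex:f7f9` -/
example (h_rax : u.reg .rax = rax) (h_rcx : u.reg .rcx = rcx) (h_rdx : u.reg .rdx = rdx) (h_rbx : u.reg .rbx = rbx) (h_rsp : u.reg .rsp = rsp) (h_rbp : u.reg .rbp = rbp) (h_rsi : u.reg .rsi = rsi) (h_rdi : u.reg .rdi = rdi) (h_r8 : u.reg .r8 = r8) (h_r9 : u.reg .r9 = r9) (h_r10 : u.reg .r10 = r10) (h_r11 : u.reg .r11 = r11) (h_r12 : u.reg .r12 = r12) (h_r13 : u.reg .r13 = r13) (h_r14 : u.reg .r14 = r14) (h_r15 : u.reg .r15 = r15) (h_rip : u.rip = 0x100000) (h_fl : u.flags = fl) (hμ : μ.vendor = .intel)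
    (hHas : ∀ a n, L.Has a n) (hCan : ∀ a : Word, a < 0x40000000)
    (hNF : ∀ {α : Type} (x : Option α), x ≠ none) (hfam : μ.cfg.field Feature.familyId = 6) (hQ : ∀ v, Q v) :
    InsnGoal L μ u Q (insn% [0xf7, 0xf9]) := by
  u_insn [h_rax, h_rcx, h_rdx, h_rbx, h_rsp, h_rbp, h_rsi, h_rdi, h_r8, h_r9, h_r10, h_r11, h_r12, h_r13, h_r14, h_r15, h_rip, h_fl, hμ]
  all_goals first | exact hHas _ _ | exact hCan _ | exact hNF _ hopt1 | exact Or.inl hfam | exact hQ _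

/-- `hex:450f47e5` -/
example (h_rax : u.reg .rax = rax) (h_rcx : u.reg .rcx = rcx) (h_rdx : u.reg .rdx = rdx) (h_rbx : u.reg .rbx = rbx) (h_rsp : u.reg .rsp = rsp) (h_rbp : u.reg .rbp = rbp) (h_rsi : u.reg .rsi = rsi) (h_rdi : u.reg .rdi = rdi) (h_r8 : u.reg .r8 = r8) (h_r9 : u.reg .r9 = r9) (h_r10 : u.reg .r10 = r10) (h_r11 : u.reg .r11 = r11) (h_r12 : u.reg .r12 = r12) (h_r13 : u.reg .r13 = r13) (h_r14 : u.reg .r14 = r14) (h_r15 : u.reg .r15 = r15) (h_rip : u.rip = 0x100000) (h_fl : u.flags = fl) (hμ : μ.vendor = .intel)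
    (hHas : ∀ a n, L.Has a n) (hCan : ∀ a : Word, a < 0x40000000)
    (hNF : ∀ {α : Type} (x : Option α), x ≠ none) (hfam : μ.cfg.field Feature.familyId = 6) (hQ : ∀ v, Q v) :
    InsnGoal L μ u Q (insn% [0x45, 0x0f, 0x47, 0xe5]) := by
  u_insn [h_rax, h_rcx, h_rdx, h_rbx, h_rsp, h_rbp, h_rsi, h_rdi, h_r8, h_r9, h_r10, h_r11, h_r12, h_r13, h_r14, h_r15, h_rip, h_fl, hμ]
  all_goals first | exact hHas _ _ | exact hCan _ | exact hNF _ hopt1 | exact Or.inl hfam | exact hQ _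

/-- `hex:09d0` -/
example (h_rax : u.reg .rax = rax) (h_rcx : u.reg .rcx = rcx) (h_rdx : u.reg .rdx = rdx) (h_rbx : u.reg .rbx = rbx) (h_rsp : u.reg .rsp = rsp) (h_rbp : u.reg .rbp = rbp) (h_rsi : u.reg .rsi = rsi) (h_rdi : u.reg .rdi = rdi) (h_r8 : u.reg .r8 = r8) (h_r9 : u.reg .r9 = r9) (h_r10 : u.reg .r10 = r10) (h_r11 : u.reg .r11 = r11) (h_r12 : u.reg .r12 = r12) (h_r13 : u.reg .r13 = r13) (h_r14 : u.reg .r14 = r14) (h_r15 : u.reg .r15 = r15) (h_rip : u.rip = 0x100000) (h_fl : u.flags = fl) (hμ : μ.vendor = .intel)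
    (hHas : ∀ a n, L.Has a n) (hCan : ∀ a : Word, a < 0x40000000)
    (hNF : ∀ {α : Type} (x : Option α), x ≠ none) (hfam : μ.cfg.field Feature.familyId = 6) (hQ : ∀ v, Q v) :
    InsnGoal L μ u Q (insn% [0x09, 0xd0]) := by
  u_insn [h_rax, h_rcx, h_rdx, h_rbx, h_rsp, h_rbp, h_rsi, h_rdi, h_r8, h_r9, h_r10, h_r11, h_r12, h_r13, h_r14, h_r15, h_rip, h_fl, hμ]
  all_goals first | exact hHas _ _ | exact hCan _ | exact hNF _ hopt1 | exact Or.inl hfam | exact hQ _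

/-- `hex:f7d9` -/
example (h_rax : u.reg .rax = rax) (h_rcx : u.reg .rcx = rcx) (h_rdx : u.reg .rdx = rdx) (h_rbx : u.reg .rbx = rbx) (h_rsp : u.reg .rsp = rsp) (h_rbp : u.reg .rbp = rbp) (h_rsi : u.reg .rsi = rsi) (h_rdi : u.reg .rdi = rdi) (h_r8 : u.reg .r8 = r8) (h_r9 : u.reg .r9 = r9) (h_r10 : u.reg .r10 = r10) (h_r11 : u.reg .r11 = r11) (h_r12 : u.reg .r12 = r12) (h_r13 : u.reg .r13 = r13) (h_r14 : u.reg .r14 = r14) (h_r15 : u.reg .r15 = r15) (h_rip : u.rip = 0x100000) (h_fl : u.flags = fl) (hμ : μ.vendor = .intel)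
    (hHas : ∀ a n, L.Has a n) (hCan : ∀ a : Word, a < 0x40000000)
    (hNF : ∀ {α : Type} (x : Option α), x ≠ none) (hfam : μ.cfg.field Feature.familyId = 6) (hQ : ∀ v, Q v) :
    InsnGoal L μ u Q (insn% [0xf7, 0xd9]) := by
  u_insn [h_rax, h_rcx, h_rdx, h_rbx, h_rsp, h_rbp, h_rsi, h_rdi, h_r8, h_r9, h_r10, h_r11, h_r12, h_r13, h_r14, h_r15, h_rip, h_fl, hμ]
  all_goals first | exact hHas _ _ | exact hCan _ | exact hNF _ hopt1 | exact Or.inl hfam | exact hQ _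

/-- `hex:f7f3` -/
example (h_rax : u.reg .rax = rax) (h_rcx : u.reg .rcx = rcx) (h_rdx : u.reg .rdx = rdx) (h_rbx : u.reg .rbx = rbx) (h_rsp : u.reg .rsp = rsp) (h_rbp : u.reg .rbp = rbp) (h_rsi : u.reg .rsi = rsi) (h_rdi : u.reg .rdi = rdi) (h_r8 : u.reg .r8 = r8) (h_r9 : u.reg .r9 = r9) (h_r10 : u.reg .r10 = r10) (h_r11 : u.reg .r11 = r11) (h_r12 : u.reg .r12 = r12) (h_r13 : u.reg .r13 = r13) (h_r14 : u.reg .r14 = r14) (h_r15 : u.reg .r15 = r15) (h_rip : u.rip = 0x100000) (h_fl : u.flags = fl) (hμ : μ.vendor = .intel)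
    (hHas : ∀ a n, L.Has a n) (hCan : ∀ a : Word, a < 0x40000000)
    (hNF : ∀ {α : Type} (x : Option α), x ≠ none) (hfam : μ.cfg.field Feature.familyId = 6) (hQ : ∀ v, Q v) :
    InsnGoal L μ u Q (insn% [0xf7, 0xf3]) := by
  u_insn [h_rax, h_rcx, h_rdx, h_rbx, h_rsp, h_rbp, h_rsi, h_rdi, h_r8, h_r9, h_r10, h_r11, h_r12, h_r13, h_r14, h_r15, h_rip, h_fl, hμ]
  all_goals first | exact hHas _ _ | exact hCan _ | exact hNF _ hopt1 | exact Or.inl hfam | exact hQ _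

/-- `hex:ffd0` -/
example (h_rax : u.reg .rax = rax) (h_rcx : u.reg .rcx = rcx) (h_rdx : u.reg .rdx = rdx) (h_rbx : u.reg .rbx = rbx) (h_rsp : u.reg .rsp = rsp) (h_rbp : u.reg .rbp = rbp) (h_rsi : u.reg .rsi = rsi) (h_rdi : u.reg .rdi = rdi) (h_r8 : u.reg .r8 = r8) (h_r9 : u.reg .r9 = r9) (h_r10 : u.reg .r10 = r10) (h_r11 : u.reg .r11 = r11) (h_r12 : u.reg .r12 = r12) (h_r13 : u.reg .r13 = r13) (h_r14 : u.reg .r14 = r14) (h_r15 : u.reg .r15 = r15) (h_rip : u.rip = 0x100000) (h_fl : u.flags = fl) (hμ : μ.vendor = .intel)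
    (hHas : ∀ a n, L.Has a n) (hCan : ∀ a : Word, a < 0x40000000)
    (hNF : ∀ {α : Type} (x : Option α), x ≠ none) (hfam : μ.cfg.field Feature.familyId = 6) (hQ : ∀ v, Q v) :
    InsnGoal L μ u Q (insn% [0xff, 0xd0]) := by
  u_insn [h_rax, h_rcx, h_rdx, h_rbx, h_rsp, h_rbp, h_rsi, h_rdi, h_r8, h_r9, h_r10, h_r11, h_r12, h_r13, h_r14, h_r15, h_rip, h_fl, hμ]
  all_goals first | exact hHas _ _ | exact hCan _ | exact hNF _ hopt1 | exact Or.inl hfam | exact hQ _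

/-- `hex:f7e3` -/
example (h_rax : u.reg .rax = rax) (h_rcx : u.reg .rcx = rcx) (h_rdx : u.reg .rdx = rdx) (h_rbx : u.reg .rbx = rbx) (h_rsp : u.reg .rsp = rsp) (h_rbp : u.reg .rbp = rbp) (h_rsi : u.reg .rsi = rsi) (h_rdi : u.reg .rdi = rdi) (h_r8 : u.reg .r8 = r8) (h_r9 : u.reg .r9 = r9) (h_r10 : u.reg .r10 = r10) (h_r11 : u.reg .r11 = r11) (h_r12 : u.reg .r12 = r12) (h_r13 : u.reg .r13 = r13) (h_r14 : u.reg .r14 = r14) (h_r15 : u.reg .r15 = r15) (h_rip : u.rip = 0x100000) (h_fl : u.flags = fl) (hμ : μ.vendor = .intel)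
    (hHas : ∀ a n, L.Has a n) (hCan : ∀ a : Word, a < 0x40000000)
    (hNF : ∀ {α : Type} (x : Option α), x ≠ none) (hfam : μ.cfg.field Feature.familyId = 6) (hQ : ∀ v, Q v) :
    InsnGoal L μ u Q (insn% [0xf7, 0xe3]) := by
  u_insn [h_rax, h_rcx, h_rdx, h_rbx, h_rsp, h_rbp, h_rsi, h_rdi, h_r8, h_r9, h_r10, h_r11, h_r12, h_r13, h_r14, h_r15, h_rip, h_fl, hμ]
  all_goals first | exact hHas _ _ | exact hCan _ | exact hNF _ hopt1 | exact Or.inl hfam | exact hQ _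

/-- `hex:31d3` -/
example (h_rax : u.reg .rax = rax) (h_rcx : u.reg .rcx = rcx) (h_rdx : u.reg .rdx = rdx) (h_rbx : u.reg .rbx = rbx) (h_rsp : u.reg .rsp = rsp) (h_rbp : u.reg .rbp = rbp) (h_rsi : u.reg .rsi = rsi) (h_rdi : u.reg .rdi = rdi) (h_r8 : u.reg .r8 = r8) (h_r9 : u.reg .r9 = r9) (h_r10 : u.reg .r10 = r10) (h_r11 : u.reg .r11 = r11) (h_r12 : u.reg .r12 = r12) (h_r13 : u.reg .r13 = r13) (h_r14 : u.reg .r14 = r14) (h_r15 : u.reg .r15 = r15) (h_rip : u.rip = 0x100000) (h_fl : u.flags = fl) (hμ : μ.vendor = .intel)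
    (hHas : ∀ a n, L.Has a n) (hCan : ∀ a : Word, a < 0x40000000)
    (hNF : ∀ {α : Type} (x : Option α), x ≠ none) (hfam : μ.cfg.field Feature.familyId = 6) (hQ : ∀ v, Q v) :
    InsnGoal L μ u Q (insn% [0x31, 0xd3]) := by
  u_insn [h_rax, h_rcx, h_rdx, h_rbx, h_rsp, h_rbp, h_rsi, h_rdi, h_r8, h_r9, h_r10, h_r11, h_r12, h_r13, h_r14, h_r15, h_rip, h_fl, hμ]
  all_goals first | exact hHas _ _ | exact hCan _ | exact hNF _ hopt1 | exact Or.inl hfam | exact hQ _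

/-- `hex:4898` -/
example (h_rax : u.reg .rax = rax) (h_rcx : u.reg .rcx = rcx) (h_rdx : u.reg .rdx = rdx) (h_rbx : u.reg .rbx = rbx) (h_rsp : u.reg .rsp = rsp) (h_rbp : u.reg .rbp = rbp) (h_rsi : u.reg .rsi = rsi) (h_rdi : u.reg .rdi = rdi) (h_r8 : u.reg .r8 = r8) (h_r9 : u.reg .r9 = r9) (h_r10 : u.reg .r10 = r10) (h_r11 : u.reg .r11 = r11) (h_r12 : u.reg .r12 = r12) (h_r13 : u.reg .r13 = r13) (h_r14 : u.reg .r14 = r14) (h_r15 : u.reg .r15 = r15) (h_rip : u.rip = 0x100000) (h_fl : u.flags = fl) (hμ : μ.vendor = .intel)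
    (hHas : ∀ a n, L.Has a n) (hCan : ∀ a : Word, a < 0x40000000)
    (hNF : ∀ {α : Type} (x : Option α), x ≠ none) (hfam : μ.cfg.field Feature.familyId = 6) (hQ : ∀ v, Q v) :
    InsnGoal L μ u Q (insn% [0x48, 0x98]) := by
  u_insn [h_rax, h_rcx, h_rdx, h_rbx, h_rsp, h_rbp, h_rsi, h_rdi, h_r8, h_r9, h_r10, h_r11, h_r12, h_r13, h_r14, h_r15, h_rip, h_fl, hμ]
  all_goals first | exact hHas _ _ | exact hCan _ | exact hNF _ hopt1 | exact Or.inl hfam | exact hQ _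

/-- `hex:c3` -/
example (h_rax : u.reg .rax = rax) (h_rcx : u.reg .rcx = rcx) (h_rdx : u.reg .rdx = rdx) (h_rbx : u.reg .rbx = rbx) (h_rsp : u.reg .rsp = rsp) (h_rbp : u.reg .rbp = rbp) (h_rsi : u.reg .rsi = rsi) (h_rdi : u.reg .rdi = rdi) (h_r8 : u.reg .r8 = r8) (h_r9 : u.reg .r9 = r9) (h_r10 : u.reg .r10 = r10) (h_r11 : u.reg .r11 = r11) (h_r12 : u.reg .r12 = r12) (h_r13 : u.reg .r13 = r13) (h_r14 : u.reg .r14 = r14) (h_r15 : u.reg .r15 = r15) (h_rip : u.rip = 0x100000) (h_fl : u.flags = fl) (hμ : μ.vendor = .intel)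
    (hHas : ∀ a n, L.Has a n) (hCan : ∀ a : Word, a < 0x40000000)
    (hNF : ∀ {α : Type} (x : Option α), x ≠ none) (hfam : μ.cfg.field Feature.familyId = 6) (hQ : ∀ v, Q v) :
    InsnGoal L μ u Q (insn% [0xc3]) := by
  u_insn [h_rax, h_rcx, h_rdx, h_rbx, h_rsp, h_rbp, h_rsi, h_rdi, h_r8, h_r9, h_r10, h_r11, h_r12, h_r13, h_r14, h_r15, h_rip, h_fl, hμ]
  all_goals first | exact hHas _ _ | exact hCan _ | exact hNF _ hopt1 | exact Or.inl hfam | exact hQ _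

/-- `hex:99` -/
example (h_rax : u.reg .rax = rax) (h_rcx : u.reg .rcx = rcx) (h_rdx : u.reg .rdx = rdx) (h_rbx : u.reg .rbx = rbx) (h_rsp : u.reg .rsp = rsp) (h_rbp : u.reg .rbp = rbp) (h_rsi : u.reg .rsi = rsi) (h_rdi : u.reg .rdi = rdi) (h_r8 : u.reg .r8 = r8) (h_r9 : u.reg .r9 = r9) (h_r10 : u.reg .r10 = r10) (h_r11 : u.reg .r11 = r11) (h_r12 : u.reg .r12 = r12) (h_r13 : u.reg .r13 = r13) (h_r14 : u.reg .r14 = r14) (h_r15 : u.reg .r15 = r15) (h_rip : u.rip = 0x100000) (h_fl : u.flags = fl) (hμ : μ.vendor = .intel)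
    (hHas : ∀ a n, L.Has a n) (hCan : ∀ a : Word, a < 0x40000000)
    (hNF : ∀ {α : Type} (x : Option α), x ≠ none) (hfam : μ.cfg.field Feature.familyId = 6) (hQ : ∀ v, Q v) :
    InsnGoal L μ u Q (insn% [0x99]) := by
  u_insn [h_rax, h_rcx, h_rdx, h_rbx, h_rsp, h_rbp, h_rsi, h_rdi, h_r8, h_r9, h_r10, h_r11, h_r12, h_r13, h_r14, h_r15, h_rip, h_fl, hμ]
  all_goals first | exact hHas _ _ | exact hCan _ | exact hNF _ hopt1 | exact Or.inl hfam | exact hQ _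

/-- `hex:c1c010` -/
example (h_rax : u.reg .rax = rax) (h_rcx : u.reg .rcx = rcx) (h_rdx : u.reg .rdx = rdx) (h_rbx : u.reg .rbx = rbx) (h_rsp : u.reg .rsp = rsp) (h_rbp : u.reg .rbp = rbp) (h_rsi : u.reg .rsi = rsi) (h_rdi : u.reg .rdi = rdi) (h_r8 : u.reg .r8 = r8) (h_r9 : u.reg .r9 = r9) (h_r10 : u.reg .r10 = r10) (h_r11 : u.reg .r11 = r11) (h_r12 : u.reg .r12 = r12) (h_r13 : u.reg .r13 = r13) (h_r14 : u.reg .r14 = r14) (h_r15 : u.reg .r15 = r15) (h_rip : u.rip = 0x100000) (h_fl : u.flags = fl) (hμ : μ.vendor = .intel)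
    (hHas : ∀ a n, L.Has a n) (hCan : ∀ a : Word, a < 0x40000000)
    (hNF : ∀ {α : Type} (x : Option α), x ≠ none) (hfam : μ.cfg.field Feature.familyId = 6) (hQ : ∀ v, Q v) :
    InsnGoal L μ u Q (insn% [0xc1, 0xc0, 0x10]) := by
  u_insn [h_rax, h_rcx, h_rdx, h_rbx, h_rsp, h_rbp, h_rsi, h_rdi, h_r8, h_r9, h_r10, h_r11, h_r12, h_r13, h_r14, h_r15, h_rip, h_fl, hμ]
  all_goals first | exact hHas _ _ | exact hCan _ | exact hNF _ hopt1 | exact Or.inl hfam | exact hQ _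

/-! ### LOCKed accesses -/

/-- `xchg dword ptr [rdi], eax` — XCHG with memory is a LOCKed access: a plain one in the user relation (`Core.moOff`). -/
example (h_rax : u.reg .rax = rax) (h_rcx : u.reg .rcx = rcx) (h_rdx : u.reg .rdx = rdx) (h_rbx : u.reg .rbx = rbx) (h_rsp : u.reg .rsp = rsp) (h_rbp : u.reg .rbp = rbp) (h_rsi : u.reg .rsi = rsi) (h_rdi : u.reg .rdi = rdi) (h_r8 : u.reg .r8 = r8) (h_r9 : u.reg .r9 = r9) (h_r10 : u.reg .r10 = r10) (h_r11 : u.reg .r11 = r11) (h_r12 : u.reg .r12 = r12) (h_r13 : u.reg .r13 = r13) (h_r14 : u.reg .r14 = r14) (h_r15 : u.reg .r15 = r15) (h_rip : u.rip = 0x100000) (h_fl : u.flags = fl) (hμ : μ.vendor = .intel)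
    (hHas : ∀ a n, L.Has a n) (hCan : ∀ a : Word, a < 0x40000000)
    (hNF : ∀ {α : Type} (x : Option α), x ≠ none) (hfam : μ.cfg.field Feature.familyId = 6) (hQ : ∀ v, Q v) :
    InsnGoal L μ u Q (insn% [0x87, 0x07]) := by
  u_insn [h_rax, h_rcx, h_rdx, h_rbx, h_rsp, h_rbp, h_rsi, h_rdi, h_r8, h_r9, h_r10, h_r11, h_r12, h_r13, h_r14, h_r15, h_rip, h_fl, hμ]
  all_goals first | exact hHas _ _ | exact hCan _ | exact hNF _ hopt1 | exact Or.inl hfam | exact hQ _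

/-- `lock add dword ptr [rdi], eax` — a LOCKed read-modify-write: the same state as `add dword ptr [rdi], eax`. -/
example (h_rax : u.reg .rax = rax) (h_rcx : u.reg .rcx = rcx) (h_rdx : u.reg .rdx = rdx) (h_rbx : u.reg .rbx = rbx) (h_rsp : u.reg .rsp = rsp) (h_rbp : u.reg .rbp = rbp) (h_rsi : u.reg .rsi = rsi) (h_rdi : u.reg .rdi = rdi) (h_r8 : u.reg .r8 = r8) (h_r9 : u.reg .r9 = r9) (h_r10 : u.reg .r10 = r10) (h_r11 : u.reg .r11 = r11) (h_r12 : u.reg .r12 = r12) (h_r13 : u.reg .r13 = r13) (h_r14 : u.reg .r14 = r14) (h_r15 : u.reg .r15 = r15) (h_rip : u.rip = 0x100000) (h_fl : u.flags = fl) (hμ : μ.vendor = .intel)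
    (hHas : ∀ a n, L.Has a n) (hCan : ∀ a : Word, a < 0x40000000)
    (hNF : ∀ {α : Type} (x : Option α), x ≠ none) (hfam : μ.cfg.field Feature.familyId = 6) (hQ : ∀ v, Q v) :
    InsnGoal L μ u Q (insn% [0xf0, 0x01, 0x07]) := by
  u_insn [h_rax, h_rcx, h_rdx, h_rbx, h_rsp, h_rbp, h_rsi, h_rdi, h_r8, h_r9, h_r10, h_r11, h_r12, h_r13, h_r14, h_r15, h_rip, h_fl, hμ]
  all_goals first | exact hHas _ _ | exact hCan _ | exact hNF _ hopt1 | exact Or.inl hfam | exact hQ _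

/-- `lock cmpxchg dword ptr [rdi], ecx` — a LOCKed read-modify-write: three continuations (equal; not equal, either microarchitecture). -/
example (h_rax : u.reg .rax = rax) (h_rcx : u.reg .rcx = rcx) (h_rdx : u.reg .rdx = rdx) (h_rbx : u.reg .rbx = rbx) (h_rsp : u.reg .rsp = rsp) (h_rbp : u.reg .rbp = rbp) (h_rsi : u.reg .rsi = rsi) (h_rdi : u.reg .rdi = rdi) (h_r8 : u.reg .r8 = r8) (h_r9 : u.reg .r9 = r9) (h_r10 : u.reg .r10 = r10) (h_r11 : u.reg .r11 = r11) (h_r12 : u.reg .r12 = r12) (h_r13 : u.reg .r13 = r13) (h_r14 : u.reg .r14 = r14) (h_r15 : u.reg .r15 = r15) (h_rip : u.rip = 0x100000) (h_fl : u.flags = fl) (hμ : μ.vendor = .intel)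
    (hHas : ∀ a n, L.Has a n) (hCan : ∀ a : Word, a < 0x40000000)
    (hNF : ∀ {α : Type} (x : Option α), x ≠ none) (hfam : μ.cfg.field Feature.familyId = 6) (hQ : ∀ v, Q v) :
    InsnGoal L μ u Q (insn% [0xf0, 0x0f, 0xb1, 0x0f]) := by
  u_insn [h_rax, h_rcx, h_rdx, h_rbx, h_rsp, h_rbp, h_rsi, h_rdi, h_r8, h_r9, h_r10, h_r11, h_r12, h_r13, h_r14, h_r15, h_rip, h_fl, hμ]
  all_goals first | exact hHas _ _ | exact hCan _ | exact hNF _ hopt1 | exact Or.inl hfam | exact hQ _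

/-! ### Forms that do not get through -/

/-- `hlt` — leaves the user subset: `L.cpl = 0` is asked, then a write of `RegRef.activity` (system state). -/
example (h_rax : u.reg .rax = rax) (h_rcx : u.reg .rcx = rcx) (h_rdx : u.reg .rdx = rdx) (h_rbx : u.reg .rbx = rbx) (h_rsp : u.reg .rsp = rsp) (h_rbp : u.reg .rbp = rbp) (h_rsi : u.reg .rsi = rsi) (h_rdi : u.reg .rdi = rdi) (h_r8 : u.reg .r8 = r8) (h_r9 : u.reg .r9 = r9) (h_r10 : u.reg .r10 = r10) (h_r11 : u.reg .r11 = r11) (h_r12 : u.reg .r12 = r12) (h_r13 : u.reg .r13 = r13) (h_r14 : u.reg .r14 = r14) (h_r15 : u.reg .r15 = r15) (h_rip : u.rip = 0x100000) (h_fl : u.flags = fl) (hμ : μ.vendor = .intel) : True := by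
  u_expect_blocked (InsnGoal L μ u Q (insn% [0xf4])) [h_rax, h_rcx, h_rdx, h_rbx, h_rsp, h_rbp, h_rsi, h_rdi, h_r8, h_r9, h_r10, h_r11, h_r12, h_r13, h_r14, h_r15, h_rip, h_fl, hμ]
  trivial

/-- `ud2` — raises #UD: the goal is `False`. -/
example (h_rax : u.reg .rax = rax) (h_rcx : u.reg .rcx = rcx) (h_rdx : u.reg .rdx = rdx) (h_rbx : u.reg .rbx = rbx) (h_rsp : u.reg .rsp = rsp) (h_rbp : u.reg .rbp = rbp) (h_rsi : u.reg .rsi = rsi) (h_rdi : u.reg .rdi = rdi) (h_r8 : u.reg .r8 = r8) (h_r9 : u.reg .r9 = r9) (h_r10 : u.reg .r10 = r10) (h_r11 : u.reg .r11 = r11) (h_r12 : u.reg .r12 = r12) (h_r13 : u.reg .r13 = r13) (h_r14 : u.reg .r14 = r14) (h_r15 : u.reg .r15 = r15) (h_rip : u.rip = 0x100000) (h_fl : u.flags = fl) (hμ : μ.vendor = .intel) : True := by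
  u_expect_blocked (InsnGoal L μ u Q (insn% [0x0f, 0x0b])) [h_rax, h_rcx, h_rdx, h_rbx, h_rsp, h_rbp, h_rsi, h_rdi, h_r8, h_r9, h_r10, h_r11, h_r12, h_r13, h_r14, h_r15, h_rip, h_fl, hμ]
  trivial

/-- `hex:f4` — as `hlt`: the image's exit is the HLT not yet executed. -/
example (h_rax : u.reg .rax = rax) (h_rcx : u.reg .rcx = rcx) (h_rdx : u.reg .rdx = rdx) (h_rbx : u.reg .rbx = rbx) (h_rsp : u.reg .rsp = rsp) (h_rbp : u.reg .rbp = rbp) (h_rsi : u.reg .rsi = rsi) (h_rdi : u.reg .rdi = rdi) (h_r8 : u.reg .r8 = r8) (h_r9 : u.reg .r9 = r9) (h_r10 : u.reg .r10 = r10) (h_r11 : u.reg .r11 = r11) (h_r12 : u.reg .r12 = r12) (h_r13 : u.reg .r13 = r13) (h_r14 : u.reg .r14 = r14) (h_r15 : u.reg .r15 = r15) (h_rip : u.rip = 0x100000) (h_fl : u.flags = fl) (hμ : μ.vendor = .intel) : True := by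
  u_expect_blocked (InsnGoal L μ u Q (insn% [0xf4])) [h_rax, h_rcx, h_rdx, h_rbx, h_rsp, h_rbp, h_rsi, h_rdi, h_r8, h_r9, h_r10, h_r11, h_r12, h_r13, h_r14, h_r15, h_rip, h_fl, hμ]
  trivial

end
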